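/- GENERATED by farm/mkassembly.py from farm/units.tsv, farm/splits.tsv and the statements of Vorbis/Spec/Units — do not edit.
   THE ASSEMBLY: from the statements of the leaf units to the end theorem for the image of the theorems.

       Final.Leaves            the statements of the 350 leaf units (99 whole functions, 251 segments,
                               0 compositions), one field each: THE HYPOTHESES of the assembly
       Assembly.stmt_<id>      the statements of the 37 split parents, by Vorbis/Spec/Splits/<id>.lean
       Assembly.seg_<id>       the claim of a segment unit at `Lay μ u₀`           | one theorem per top-level unit (239), bottom-up:
       Assembly.ctr_<fn>       the contract of a function as its callers assume it | the unit's statement applied to `AllCode`'s field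
                               and to the theorems of its dependencies
       the 17 COMPOSITION units  are NOT fields: their accepted proofs are in the tree (Vorbis/Spec/Worked/<id>.lean) and are used
       Assembly.closedTop      `Final.ClosedTop Lay μ u₀`: the contracts of `run_ctors` and `decode_all`, no hypothesis left
       Final.assembly          `Leaves → VorbisStaysInCode (symbols.image imageV5)`, by `Final.v5` (= `Final.of_top` at
                               `Final.imageFacts_v5`) from the stub's statement and `closedTop`
   What the shared binders are discharged with: `Lay`, `Lay.hi = 0x1000000`, `μ`, `UserX.MicroOK μ`, `u₀`, `AllCode Lay u₀` are
   bound by `Final.of_top`'s hypothesis `hclosed` (it instantiates them: the start layout, `startLayout_hi`, the end theorem's own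
   processor hypothesis, the start state, `ImageFacts.code`). -/
import Vorbis.Spec.AllUnits
import Vorbis.Spec.Alloc
import Vorbis.Spec.FinalImage
import Vorbis.Spec.Splits.codebook_decode_deinterleave_repeat_2
import Vorbis.Spec.Splits.compute_codewords
import Vorbis.Spec.Splits.decode_all
import Vorbis.Spec.Splits.decode_residue_1
import Vorbis.Spec.Splits.decode_residue_4
import Vorbis.Spec.Splits.decode_residue_6
import Vorbis.Spec.Splits.decode_residue_6b
import Vorbis.Spec.Splits.decode_residue_7
import Vorbis.Spec.Splits.inverse_mdct_7
import Vorbis.Spec.Splits.start_decoder_2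
import Vorbis.Spec.Splits.start_decoder_9
import Vorbis.Spec.Splits.start_decoder_C11
import Vorbis.Spec.Splits.start_decoder_C13
import Vorbis.Spec.Splits.start_decoder_C14
import Vorbis.Spec.Splits.start_decoder_C2
import Vorbis.Spec.Splits.start_decoder_C3
import Vorbis.Spec.Splits.start_decoder_C4
import Vorbis.Spec.Splits.start_decoder_C5
import Vorbis.Spec.Splits.start_decoder_C6
import Vorbis.Spec.Splits.start_decoder_C7
import Vorbis.Spec.Splits.start_decoder_C8
import Vorbis.Spec.Splits.start_decoder_C9
import Vorbis.Spec.Splits.start_decoder_F2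
import Vorbis.Spec.Splits.start_decoder_F4
import Vorbis.Spec.Splits.start_decoder_F5
import Vorbis.Spec.Splits.start_decoder_F6
import Vorbis.Spec.Splits.start_decoder_R1
import Vorbis.Spec.Splits.start_decoder_R12
import Vorbis.Spec.Splits.start_decoder_R7
import Vorbis.Spec.Splits.stb_vorbis_get_frame_float
import Vorbis.Spec.Splits.vorbis_decode_initial
import Vorbis.Spec.Splits.vorbis_decode_packet_rest_1
import Vorbis.Spec.Splits.vorbis_decode_packet_rest_2
import Vorbis.Spec.Splits.vorbis_decode_packet_rest_3
import Vorbis.Spec.Splits.vorbis_decode_packet_rest_4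
import Vorbis.Spec.Splits.vorbis_decode_packet_rest_5
import Vorbis.Spec.Splits.vorbis_finish_frame
import Vorbis.Spec.Worked.codebook_decode_deinterleave_repeat_COMPOSITION
import Vorbis.Spec.Worked.codebook_decode_scalar_raw_COMPOSITION
import Vorbis.Spec.Worked.compute_codewords_COMPOSITION
import Vorbis.Spec.Worked.compute_sorted_huffman_COMPOSITION
import Vorbis.Spec.Worked.decode_all_COMPOSITION
import Vorbis.Spec.Worked.decode_residue_COMPOSITION
import Vorbis.Spec.Worked.imdct_step3_inner_r_loop_COMPOSITION
import Vorbis.Spec.Worked.imdct_step3_inner_s_loop_COMPOSITION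
import Vorbis.Spec.Worked.imdct_step3_inner_s_loop_ld654_COMPOSITION
import Vorbis.Spec.Worked.imdct_step3_iter0_loop_COMPOSITION
import Vorbis.Spec.Worked.inverse_mdct_COMPOSITION
import Vorbis.Spec.Worked.start_decoder_COMPOSITION
import Vorbis.Spec.Worked.stb_vorbis_get_frame_float_COMPOSITION
import Vorbis.Spec.Worked.vorbis_decode_initial_COMPOSITION
import Vorbis.Spec.Worked.vorbis_decode_packet_rest_COMPOSITION
import Vorbis.Spec.Worked.vorbis_deinit_COMPOSITION
import Vorbis.Spec.Worked.vorbis_finish_frame_COMPOSITION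
namespace Vorbis.Spec
open X86 X86.User Asan

/-- **The statements of the LEAF units** (a leaf: a unit that is neither a split parent nor a composition with a tree copy):
what the assembly takes as given. Whether a leaf is PROVED is bookkeeping outside this file (the farm's verdicts); the value of
this structure is built from the accepted proofs by a second generated file. One field per unit, named by the unit's Lean id. -/
structure Final.Leaves : Prop where
  /-- unit `__asan_register_globals`: a whole function -/
  h_asan_register_globals : Vorbis.Spec.asan_register_globals.Statement
  /-- unit `_sub_I_65535_1`: a whole function -/
  h_sub_I_65535_1 : Vorbis.Spec.sub_I_65535_1.Statement
  /-- unit `run_ctors`: a whole function -/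
  h_run_ctors : Vorbis.Spec.run_ctors.Statement
  /-- unit `__asan_load4_noabort`: a whole function -/
  h_asan_load4_noabort : Vorbis.Spec.asan_load4_noabort.Statement
  /-- unit `__asan_store4_noabort`: a whole function -/
  h_asan_store4_noabort : Vorbis.Spec.asan_store4_noabort.Statement
  /-- unit `__asan_load8_noabort`: a whole function -/
  h_asan_load8_noabort : Vorbis.Spec.asan_load8_noabort.Statement
  /-- unit `copy_frame`: a whole function -/
  h_copy_frame : Vorbis.Spec.copy_frame.Statement
  /-- unit `put_header`: a whole function -/
  h_put_header : Vorbis.Spec.put_header.Statement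
  /-- unit `free`: a whole function -/
  h_free : Vorbis.Spec.free.Statement
  /-- unit `setup_free`: a whole function -/
  h_setup_free : Vorbis.Spec.setup_free.Statement
  /-- unit `__asan_load1_noabort`: a whole function -/
  h_asan_load1_noabort : Vorbis.Spec.asan_load1_noabort.Statement
  /-- unit `vorbis_deinit.1`: a segment of `vorbis_deinit` -/
  h_vorbis_deinit_1 : Vorbis.Spec.vorbis_deinit_1.Statement
  /-- unit `vorbis_deinit.2`: a segment of `vorbis_deinit` -/
  h_vorbis_deinit_2 : Vorbis.Spec.vorbis_deinit_2.Statement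
  /-- unit `vorbis_deinit.3`: a segment of `vorbis_deinit` -/
  h_vorbis_deinit_3 : Vorbis.Spec.vorbis_deinit_3.Statement
  /-- unit `vorbis_deinit.4`: a segment of `vorbis_deinit` -/
  h_vorbis_deinit_4 : Vorbis.Spec.vorbis_deinit_4.Statement
  /-- unit `stb_vorbis_close`: a whole function -/
  h_stb_vorbis_close : Vorbis.Spec.stb_vorbis_close.Statement
  /-- unit `stb_vorbis_get_error`: a whole function -/
  h_stb_vorbis_get_error : Vorbis.Spec.stb_vorbis_get_error.Statement
  /-- unit `__asan_store8_noabort`: a whole function -/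
  h_asan_store8_noabort : Vorbis.Spec.asan_store8_noabort.Statement
  /-- unit `get_window`: a whole function -/
  h_get_window : Vorbis.Spec.get_window.Statement
  /-- unit `vorbis_finish_frame.1`: a segment of `vorbis_finish_frame`, child of the split of `vorbis_finish_frame` -/
  h_vorbis_finish_frame_1 : Vorbis.Spec.vorbis_finish_frame_1.Statement
  /-- unit `vorbis_finish_frame.2`: a segment of `vorbis_finish_frame`, child of the split of `vorbis_finish_frame` -/
  h_vorbis_finish_frame_2 : Vorbis.Spec.vorbis_finish_frame_2.Statement
  /-- unit `vorbis_finish_frame.3`: a segment of `vorbis_finish_frame`, child of the split of `vorbis_finish_frame` -/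
  h_vorbis_finish_frame_3 : Vorbis.Spec.vorbis_finish_frame_3.Statement
  /-- unit `vorbis_finish_frame.4`: a segment of `vorbis_finish_frame`, child of the split of `vorbis_finish_frame` -/
  h_vorbis_finish_frame_4 : Vorbis.Spec.vorbis_finish_frame_4.Statement
  /-- unit `vorbis_finish_frame.5`: a segment of `vorbis_finish_frame`, child of the split of `vorbis_finish_frame` -/
  h_vorbis_finish_frame_5 : Vorbis.Spec.vorbis_finish_frame_5.Statement
  /-- unit `__asan_store1_noabort`: a whole function -/
  h_asan_store1_noabort : Vorbis.Spec.asan_store1_noabort.Statement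
  /-- unit `__asan_load2_noabort`: a whole function -/
  h_asan_load2_noabort : Vorbis.Spec.asan_load2_noabort.Statement
  /-- unit `__asan_store2_noabort`: a whole function -/
  h_asan_store2_noabort : Vorbis.Spec.asan_store2_noabort.Statement
  /-- unit `memcpy`: a whole function -/
  h_memcpy : Vorbis.Spec.memcpy.Statement
  /-- unit `memset`: a whole function -/
  h_memset : Vorbis.Spec.memset.Statement
  /-- unit `error`: a whole function -/
  h_error : Vorbis.Spec.error.Statement
  /-- unit `ilog`: a whole function -/
  h_ilog : Vorbis.Spec.ilog.Statement
  /-- unit `abs`: a whole function -/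
  h_abs : Vorbis.Spec.abs.Statement
  /-- unit `predict_point`: a whole function -/
  h_predict_point : Vorbis.Spec.predict_point.Statement
  /-- unit `draw_line`: a whole function -/
  h_draw_line : Vorbis.Spec.draw_line.Statement
  /-- unit `do_floor`: a whole function -/
  h_do_floor : Vorbis.Spec.do_floor.Statement
  /-- unit `imdct_step3_iter0_loop.1`: a segment of `imdct_step3_iter0_loop` -/
  h_imdct_step3_iter0_loop_1 : Vorbis.Spec.imdct_step3_iter0_loop_1.Statement
  /-- unit `imdct_step3_iter0_loop.2`: a segment of `imdct_step3_iter0_loop` -/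
  h_imdct_step3_iter0_loop_2 : Vorbis.Spec.imdct_step3_iter0_loop_2.Statement
  /-- unit `imdct_step3_iter0_loop.3`: a segment of `imdct_step3_iter0_loop` -/
  h_imdct_step3_iter0_loop_3 : Vorbis.Spec.imdct_step3_iter0_loop_3.Statement
  /-- unit `imdct_step3_iter0_loop.4`: a segment of `imdct_step3_iter0_loop` -/
  h_imdct_step3_iter0_loop_4 : Vorbis.Spec.imdct_step3_iter0_loop_4.Statement
  /-- unit `imdct_step3_inner_r_loop.1`: a segment of `imdct_step3_inner_r_loop` -/
  h_imdct_step3_inner_r_loop_1 : Vorbis.Spec.imdct_step3_inner_r_loop_1.Statement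
  /-- unit `imdct_step3_inner_r_loop.2`: a segment of `imdct_step3_inner_r_loop` -/
  h_imdct_step3_inner_r_loop_2 : Vorbis.Spec.imdct_step3_inner_r_loop_2.Statement
  /-- unit `imdct_step3_inner_r_loop.3`: a segment of `imdct_step3_inner_r_loop` -/
  h_imdct_step3_inner_r_loop_3 : Vorbis.Spec.imdct_step3_inner_r_loop_3.Statement
  /-- unit `imdct_step3_inner_r_loop.4`: a segment of `imdct_step3_inner_r_loop` -/
  h_imdct_step3_inner_r_loop_4 : Vorbis.Spec.imdct_step3_inner_r_loop_4.Statement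
  /-- unit `imdct_step3_inner_s_loop.1`: a segment of `imdct_step3_inner_s_loop` -/
  h_imdct_step3_inner_s_loop_1 : Vorbis.Spec.imdct_step3_inner_s_loop_1.Statement
  /-- unit `imdct_step3_inner_s_loop.2`: a segment of `imdct_step3_inner_s_loop` -/
  h_imdct_step3_inner_s_loop_2 : Vorbis.Spec.imdct_step3_inner_s_loop_2.Statement
  /-- unit `imdct_step3_inner_s_loop.3`: a segment of `imdct_step3_inner_s_loop` -/
  h_imdct_step3_inner_s_loop_3 : Vorbis.Spec.imdct_step3_inner_s_loop_3.Statement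
  /-- unit `iter_54`: a whole function -/
  h_iter_54 : Vorbis.Spec.iter_54.Statement
  /-- unit `imdct_step3_inner_s_loop_ld654.1`: a segment of `imdct_step3_inner_s_loop_ld654` -/
  h_imdct_step3_inner_s_loop_ld654_1 : Vorbis.Spec.imdct_step3_inner_s_loop_ld654_1.Statement
  /-- unit `imdct_step3_inner_s_loop_ld654.2`: a segment of `imdct_step3_inner_s_loop_ld654` -/
  h_imdct_step3_inner_s_loop_ld654_2 : Vorbis.Spec.imdct_step3_inner_s_loop_ld654_2.Statement
  /-- unit `imdct_step3_inner_s_loop_ld654.3`: a segment of `imdct_step3_inner_s_loop_ld654` -/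
  h_imdct_step3_inner_s_loop_ld654_3 : Vorbis.Spec.imdct_step3_inner_s_loop_ld654_3.Statement
  /-- unit `arena_unpoison`: a whole function -/
  h_arena_unpoison : Vorbis.Spec.arena_unpoison.Statement
  /-- unit `malloc`: a whole function -/
  h_malloc : Vorbis.Spec.malloc.Statement
  /-- unit `setup_temp_malloc`: a whole function -/
  h_setup_temp_malloc : Vorbis.Spec.setup_temp_malloc.Statement
  /-- unit `arena_poison`: a whole function -/
  h_arena_poison : Vorbis.Spec.arena_poison.Statement
  /-- unit `arena_temp_restore`: a whole function -/
  h_arena_temp_restore : Vorbis.Spec.arena_temp_restore.Statement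
  /-- unit `inverse_mdct.1`: a segment of `inverse_mdct` -/
  h_inverse_mdct_1 : Vorbis.Spec.inverse_mdct_1.Statement
  /-- unit `inverse_mdct.2`: a segment of `inverse_mdct` -/
  h_inverse_mdct_2 : Vorbis.Spec.inverse_mdct_2.Statement
  /-- unit `inverse_mdct.3`: a segment of `inverse_mdct` -/
  h_inverse_mdct_3 : Vorbis.Spec.inverse_mdct_3.Statement
  /-- unit `inverse_mdct.4`: a segment of `inverse_mdct` -/
  h_inverse_mdct_4 : Vorbis.Spec.inverse_mdct_4.Statement
  /-- unit `inverse_mdct.5`: a segment of `inverse_mdct` -/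
  h_inverse_mdct_5 : Vorbis.Spec.inverse_mdct_5.Statement
  /-- unit `inverse_mdct.6`: a segment of `inverse_mdct` -/
  h_inverse_mdct_6 : Vorbis.Spec.inverse_mdct_6.Statement
  /-- unit `inverse_mdct.7a`: a segment of `inverse_mdct`, child of the split of `inverse_mdct.7` -/
  h_inverse_mdct_7a : Vorbis.Spec.inverse_mdct_7a.Statement
  /-- unit `inverse_mdct.7b`: a segment of `inverse_mdct`, child of the split of `inverse_mdct.7` -/
  h_inverse_mdct_7b : Vorbis.Spec.inverse_mdct_7b.Statement
  /-- unit `inverse_mdct.8`: a segment of `inverse_mdct` -/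
  h_inverse_mdct_8 : Vorbis.Spec.inverse_mdct_8.Statement
  /-- unit `inverse_mdct.9`: a segment of `inverse_mdct` -/
  h_inverse_mdct_9 : Vorbis.Spec.inverse_mdct_9.Statement
  /-- unit `inverse_mdct.10`: a segment of `inverse_mdct` -/
  h_inverse_mdct_10 : Vorbis.Spec.inverse_mdct_10.Statement
  /-- unit `inverse_mdct.11`: a segment of `inverse_mdct` -/
  h_inverse_mdct_11 : Vorbis.Spec.inverse_mdct_11.Statement
  /-- unit `inverse_mdct.12`: a segment of `inverse_mdct` -/
  h_inverse_mdct_12 : Vorbis.Spec.inverse_mdct_12.Statement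
  /-- unit `get8`: a whole function -/
  h_get8 : Vorbis.Spec.get8.Statement
  /-- unit `capture_pattern`: a whole function -/
  h_capture_pattern : Vorbis.Spec.capture_pattern.Statement
  /-- unit `get32`: a whole function -/
  h_get32 : Vorbis.Spec.get32.Statement
  /-- unit `getn`: a whole function -/
  h_getn : Vorbis.Spec.getn.Statement
  /-- unit `stb_vorbis_get_file_offset`: a whole function -/
  h_stb_vorbis_get_file_offset : Vorbis.Spec.stb_vorbis_get_file_offset.Statement
  /-- unit `start_page_no_capturepattern`: a whole function -/
  h_start_page_no_capturepattern : Vorbis.Spec.start_page_no_capturepattern.Statement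
  /-- unit `start_page`: a whole function -/
  h_start_page : Vorbis.Spec.start_page.Statement
  /-- unit `next_segment`: a whole function -/
  h_next_segment : Vorbis.Spec.next_segment.Statement
  /-- unit `get8_packet_raw`: a whole function -/
  h_get8_packet_raw : Vorbis.Spec.get8_packet_raw.Statement
  /-- unit `get_bits.24`: a whole function (proves `get_bits.spec24`) -/
  h_get_bits_24 : Vorbis.Spec.get_bits_24.Statement
  /-- unit `get_bits`: a whole function -/
  h_get_bits : Vorbis.Spec.get_bits.Statement
  /-- unit `prep_huffman`: a whole function -/
  h_prep_huffman : Vorbis.Spec.prep_huffman.Statement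
  /-- unit `bit_reverse`: a whole function -/
  h_bit_reverse : Vorbis.Spec.bit_reverse.Statement
  /-- unit `codebook_decode_scalar_raw.1`: a segment of `codebook_decode_scalar_raw` -/
  h_codebook_decode_scalar_raw_1 : Vorbis.Spec.codebook_decode_scalar_raw_1.Statement
  /-- unit `codebook_decode_scalar_raw.2`: a segment of `codebook_decode_scalar_raw` -/
  h_codebook_decode_scalar_raw_2 : Vorbis.Spec.codebook_decode_scalar_raw_2.Statement
  /-- unit `codebook_decode_scalar_raw.3`: a segment of `codebook_decode_scalar_raw` -/
  h_codebook_decode_scalar_raw_3 : Vorbis.Spec.codebook_decode_scalar_raw_3.Statement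
  /-- unit `codebook_decode_scalar_raw.4`: a segment of `codebook_decode_scalar_raw` -/
  h_codebook_decode_scalar_raw_4 : Vorbis.Spec.codebook_decode_scalar_raw_4.Statement
  /-- unit `make_block_array`: a whole function -/
  h_make_block_array : Vorbis.Spec.make_block_array.Statement
  /-- unit `codebook_decode_deinterleave_repeat.1`: a segment of `codebook_decode_deinterleave_repeat` -/
  h_codebook_decode_deinterleave_repeat_1 : Vorbis.Spec.codebook_decode_deinterleave_repeat_1.Statement
  /-- unit `codebook_decode_deinterleave_repeat.2a`: a segment of `codebook_decode_deinterleave_repeat`, child of the split of `codebook_decode_deinterleave_repeat.2` -/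
  h_codebook_decode_deinterleave_repeat_2a : Vorbis.Spec.codebook_decode_deinterleave_repeat_2a.Statement
  /-- unit `codebook_decode_deinterleave_repeat.2b`: a segment of `codebook_decode_deinterleave_repeat`, child of the split of `codebook_decode_deinterleave_repeat.2` -/
  h_codebook_decode_deinterleave_repeat_2b : Vorbis.Spec.codebook_decode_deinterleave_repeat_2b.Statement
  /-- unit `codebook_decode_deinterleave_repeat.2c`: a segment of `codebook_decode_deinterleave_repeat`, child of the split of `codebook_decode_deinterleave_repeat.2` -/
  h_codebook_decode_deinterleave_repeat_2c : Vorbis.Spec.codebook_decode_deinterleave_repeat_2c.Statement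
  /-- unit `codebook_decode_deinterleave_repeat.2d`: a segment of `codebook_decode_deinterleave_repeat`, child of the split of `codebook_decode_deinterleave_repeat.2` -/
  h_codebook_decode_deinterleave_repeat_2d : Vorbis.Spec.codebook_decode_deinterleave_repeat_2d.Statement
  /-- unit `codebook_decode_deinterleave_repeat.3`: a segment of `codebook_decode_deinterleave_repeat` -/
  h_codebook_decode_deinterleave_repeat_3 : Vorbis.Spec.codebook_decode_deinterleave_repeat_3.Statement
  /-- unit `codebook_decode_deinterleave_repeat.4`: a segment of `codebook_decode_deinterleave_repeat` -/
  h_codebook_decode_deinterleave_repeat_4 : Vorbis.Spec.codebook_decode_deinterleave_repeat_4.Statement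
  /-- unit `codebook_decode_deinterleave_repeat.5`: a segment of `codebook_decode_deinterleave_repeat` -/
  h_codebook_decode_deinterleave_repeat_5 : Vorbis.Spec.codebook_decode_deinterleave_repeat_5.Statement
  /-- unit `codebook_decode_deinterleave_repeat.6`: a segment of `codebook_decode_deinterleave_repeat` -/
  h_codebook_decode_deinterleave_repeat_6 : Vorbis.Spec.codebook_decode_deinterleave_repeat_6.Statement
  /-- unit `codebook_decode_deinterleave_repeat.7`: a segment of `codebook_decode_deinterleave_repeat` -/
  h_codebook_decode_deinterleave_repeat_7 : Vorbis.Spec.codebook_decode_deinterleave_repeat_7.Statement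
  /-- unit `codebook_decode_start`: a whole function -/
  h_codebook_decode_start : Vorbis.Spec.codebook_decode_start.Statement
  /-- unit `codebook_decode_step`: a whole function -/
  h_codebook_decode_step : Vorbis.Spec.codebook_decode_step.Statement
  /-- unit `codebook_decode`: a whole function -/
  h_codebook_decode : Vorbis.Spec.codebook_decode.Statement
  /-- unit `residue_decode`: a whole function -/
  h_residue_decode : Vorbis.Spec.residue_decode.Statement
  /-- unit `decode_residue.1a`: a segment of `decode_residue`, child of the split of `decode_residue.1` -/
  h_decode_residue_1a : Vorbis.Spec.decode_residue_1a.Statement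
  /-- unit `decode_residue.1b`: a segment of `decode_residue`, child of the split of `decode_residue.1` -/
  h_decode_residue_1b : Vorbis.Spec.decode_residue_1b.Statement
  /-- unit `decode_residue.1c`: a segment of `decode_residue`, child of the split of `decode_residue.1` -/
  h_decode_residue_1c : Vorbis.Spec.decode_residue_1c.Statement
  /-- unit `decode_residue.1d`: a segment of `decode_residue`, child of the split of `decode_residue.1` -/
  h_decode_residue_1d : Vorbis.Spec.decode_residue_1d.Statement
  /-- unit `decode_residue.2`: a segment of `decode_residue` -/
  h_decode_residue_2 : Vorbis.Spec.decode_residue_2.Statement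
  /-- unit `decode_residue.3`: a segment of `decode_residue` -/
  h_decode_residue_3 : Vorbis.Spec.decode_residue_3.Statement
  /-- unit `decode_residue.4a`: a segment of `decode_residue`, child of the split of `decode_residue.4` -/
  h_decode_residue_4a : Vorbis.Spec.decode_residue_4a.Statement
  /-- unit `decode_residue.4b`: a segment of `decode_residue`, child of the split of `decode_residue.4` -/
  h_decode_residue_4b : Vorbis.Spec.decode_residue_4b.Statement
  /-- unit `decode_residue.5`: a segment of `decode_residue` -/
  h_decode_residue_5 : Vorbis.Spec.decode_residue_5.Statement
  /-- unit `decode_residue.6a`: a segment of `decode_residue`, child of the split of `decode_residue.6` -/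
  h_decode_residue_6a : Vorbis.Spec.decode_residue_6a.Statement
  /-- unit `decode_residue.6ba`: a segment of `decode_residue`, child of the split of `decode_residue.6b` -/
  h_decode_residue_6ba : Vorbis.Spec.decode_residue_6ba.Statement
  /-- unit `decode_residue.6bb`: a segment of `decode_residue`, child of the split of `decode_residue.6b` -/
  h_decode_residue_6bb : Vorbis.Spec.decode_residue_6bb.Statement
  /-- unit `decode_residue.7a`: a segment of `decode_residue`, child of the split of `decode_residue.7` -/
  h_decode_residue_7a : Vorbis.Spec.decode_residue_7a.Statement
  /-- unit `decode_residue.7b`: a segment of `decode_residue`, child of the split of `decode_residue.7` -/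
  h_decode_residue_7b : Vorbis.Spec.decode_residue_7b.Statement
  /-- unit `decode_residue.7c`: a segment of `decode_residue`, child of the split of `decode_residue.7` -/
  h_decode_residue_7c : Vorbis.Spec.decode_residue_7c.Statement
  /-- unit `decode_residue.8`: a segment of `decode_residue` -/
  h_decode_residue_8 : Vorbis.Spec.decode_residue_8.Statement
  /-- unit `decode_residue.9`: a segment of `decode_residue` -/
  h_decode_residue_9 : Vorbis.Spec.decode_residue_9.Statement
  /-- unit `decode_residue.10`: a segment of `decode_residue` -/
  h_decode_residue_10 : Vorbis.Spec.decode_residue_10.Statement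
  /-- unit `decode_residue.11`: a segment of `decode_residue` -/
  h_decode_residue_11 : Vorbis.Spec.decode_residue_11.Statement
  /-- unit `flush_packet`: a whole function -/
  h_flush_packet : Vorbis.Spec.flush_packet.Statement
  /-- unit `vorbis_decode_packet_rest.1a`: a segment of `vorbis_decode_packet_rest`, child of the split of `vorbis_decode_packet_rest.1` -/
  h_vorbis_decode_packet_rest_1a : Vorbis.Spec.vorbis_decode_packet_rest_1a.Statement
  /-- unit `vorbis_decode_packet_rest.1b`: a segment of `vorbis_decode_packet_rest`, child of the split of `vorbis_decode_packet_rest.1` -/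
  h_vorbis_decode_packet_rest_1b : Vorbis.Spec.vorbis_decode_packet_rest_1b.Statement
  /-- unit `vorbis_decode_packet_rest.2a`: a segment of `vorbis_decode_packet_rest`, child of the split of `vorbis_decode_packet_rest.2` -/
  h_vorbis_decode_packet_rest_2a : Vorbis.Spec.vorbis_decode_packet_rest_2a.Statement
  /-- unit `vorbis_decode_packet_rest.2b`: a segment of `vorbis_decode_packet_rest`, child of the split of `vorbis_decode_packet_rest.2` -/
  h_vorbis_decode_packet_rest_2b : Vorbis.Spec.vorbis_decode_packet_rest_2b.Statement
  /-- unit `vorbis_decode_packet_rest.2c`: a segment of `vorbis_decode_packet_rest`, child of the split of `vorbis_decode_packet_rest.2` -/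
  h_vorbis_decode_packet_rest_2c : Vorbis.Spec.vorbis_decode_packet_rest_2c.Statement
  /-- unit `vorbis_decode_packet_rest.2d`: a segment of `vorbis_decode_packet_rest`, child of the split of `vorbis_decode_packet_rest.2` -/
  h_vorbis_decode_packet_rest_2d : Vorbis.Spec.vorbis_decode_packet_rest_2d.Statement
  /-- unit `vorbis_decode_packet_rest.3a`: a segment of `vorbis_decode_packet_rest`, child of the split of `vorbis_decode_packet_rest.3` -/
  h_vorbis_decode_packet_rest_3a : Vorbis.Spec.vorbis_decode_packet_rest_3a.Statement
  /-- unit `vorbis_decode_packet_rest.3b`: a segment of `vorbis_decode_packet_rest`, child of the split of `vorbis_decode_packet_rest.3` -/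
  h_vorbis_decode_packet_rest_3b : Vorbis.Spec.vorbis_decode_packet_rest_3b.Statement
  /-- unit `vorbis_decode_packet_rest.3c`: a segment of `vorbis_decode_packet_rest`, child of the split of `vorbis_decode_packet_rest.3` -/
  h_vorbis_decode_packet_rest_3c : Vorbis.Spec.vorbis_decode_packet_rest_3c.Statement
  /-- unit `vorbis_decode_packet_rest.4a`: a segment of `vorbis_decode_packet_rest`, child of the split of `vorbis_decode_packet_rest.4` -/
  h_vorbis_decode_packet_rest_4a : Vorbis.Spec.vorbis_decode_packet_rest_4a.Statement
  /-- unit `vorbis_decode_packet_rest.4b`: a segment of `vorbis_decode_packet_rest`, child of the split of `vorbis_decode_packet_rest.4` -/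
  h_vorbis_decode_packet_rest_4b : Vorbis.Spec.vorbis_decode_packet_rest_4b.Statement
  /-- unit `vorbis_decode_packet_rest.4c`: a segment of `vorbis_decode_packet_rest`, child of the split of `vorbis_decode_packet_rest.4` -/
  h_vorbis_decode_packet_rest_4c : Vorbis.Spec.vorbis_decode_packet_rest_4c.Statement
  /-- unit `vorbis_decode_packet_rest.4d`: a segment of `vorbis_decode_packet_rest`, child of the split of `vorbis_decode_packet_rest.4` -/
  h_vorbis_decode_packet_rest_4d : Vorbis.Spec.vorbis_decode_packet_rest_4d.Statement
  /-- unit `vorbis_decode_packet_rest.4e`: a segment of `vorbis_decode_packet_rest`, child of the split of `vorbis_decode_packet_rest.4` -/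
  h_vorbis_decode_packet_rest_4e : Vorbis.Spec.vorbis_decode_packet_rest_4e.Statement
  /-- unit `vorbis_decode_packet_rest.5a`: a segment of `vorbis_decode_packet_rest`, child of the split of `vorbis_decode_packet_rest.5` -/
  h_vorbis_decode_packet_rest_5a : Vorbis.Spec.vorbis_decode_packet_rest_5a.Statement
  /-- unit `vorbis_decode_packet_rest.5b`: a segment of `vorbis_decode_packet_rest`, child of the split of `vorbis_decode_packet_rest.5` -/
  h_vorbis_decode_packet_rest_5b : Vorbis.Spec.vorbis_decode_packet_rest_5b.Statement
  /-- unit `vorbis_decode_packet_rest.5c`: a segment of `vorbis_decode_packet_rest`, child of the split of `vorbis_decode_packet_rest.5` -/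
  h_vorbis_decode_packet_rest_5c : Vorbis.Spec.vorbis_decode_packet_rest_5c.Statement
  /-- unit `vorbis_decode_packet_rest.6`: a segment of `vorbis_decode_packet_rest` -/
  h_vorbis_decode_packet_rest_6 : Vorbis.Spec.vorbis_decode_packet_rest_6.Statement
  /-- unit `vorbis_decode_packet_rest.7`: a segment of `vorbis_decode_packet_rest` -/
  h_vorbis_decode_packet_rest_7 : Vorbis.Spec.vorbis_decode_packet_rest_7.Statement
  /-- unit `vorbis_decode_packet_rest.8`: a segment of `vorbis_decode_packet_rest` -/
  h_vorbis_decode_packet_rest_8 : Vorbis.Spec.vorbis_decode_packet_rest_8.Statement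
  /-- unit `vorbis_decode_packet_rest.9`: a segment of `vorbis_decode_packet_rest` -/
  h_vorbis_decode_packet_rest_9 : Vorbis.Spec.vorbis_decode_packet_rest_9.Statement
  /-- unit `vorbis_decode_packet_rest.10`: a segment of `vorbis_decode_packet_rest` -/
  h_vorbis_decode_packet_rest_10 : Vorbis.Spec.vorbis_decode_packet_rest_10.Statement
  /-- unit `vorbis_decode_packet_rest.11`: a segment of `vorbis_decode_packet_rest` -/
  h_vorbis_decode_packet_rest_11 : Vorbis.Spec.vorbis_decode_packet_rest_11.Statement
  /-- unit `vorbis_decode_packet_rest.12`: a segment of `vorbis_decode_packet_rest` -/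
  h_vorbis_decode_packet_rest_12 : Vorbis.Spec.vorbis_decode_packet_rest_12.Statement
  /-- unit `vorbis_decode_packet_rest.13`: a segment of `vorbis_decode_packet_rest` -/
  h_vorbis_decode_packet_rest_13 : Vorbis.Spec.vorbis_decode_packet_rest_13.Statement
  /-- unit `vorbis_decode_packet_rest.14`: a segment of `vorbis_decode_packet_rest` -/
  h_vorbis_decode_packet_rest_14 : Vorbis.Spec.vorbis_decode_packet_rest_14.Statement
  /-- unit `vorbis_decode_packet_rest.15`: a segment of `vorbis_decode_packet_rest` -/
  h_vorbis_decode_packet_rest_15 : Vorbis.Spec.vorbis_decode_packet_rest_15.Statement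
  /-- unit `vorbis_decode_packet_rest.16`: a segment of `vorbis_decode_packet_rest` -/
  h_vorbis_decode_packet_rest_16 : Vorbis.Spec.vorbis_decode_packet_rest_16.Statement
  /-- unit `get8_packet`: a whole function -/
  h_get8_packet : Vorbis.Spec.get8_packet.Statement
  /-- unit `start_packet`: a whole function -/
  h_start_packet : Vorbis.Spec.start_packet.Statement
  /-- unit `maybe_start_packet`: a whole function -/
  h_maybe_start_packet : Vorbis.Spec.maybe_start_packet.Statement
  /-- unit `vorbis_decode_initial.1`: a segment of `vorbis_decode_initial`, child of the split of `vorbis_decode_initial` -/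
  h_vorbis_decode_initial_1 : Vorbis.Spec.vorbis_decode_initial_1.Statement
  /-- unit `vorbis_decode_initial.2`: a segment of `vorbis_decode_initial`, child of the split of `vorbis_decode_initial` -/
  h_vorbis_decode_initial_2 : Vorbis.Spec.vorbis_decode_initial_2.Statement
  /-- unit `vorbis_decode_initial.3`: a segment of `vorbis_decode_initial`, child of the split of `vorbis_decode_initial` -/
  h_vorbis_decode_initial_3 : Vorbis.Spec.vorbis_decode_initial_3.Statement
  /-- unit `vorbis_decode_initial.4`: a segment of `vorbis_decode_initial`, child of the split of `vorbis_decode_initial` -/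
  h_vorbis_decode_initial_4 : Vorbis.Spec.vorbis_decode_initial_4.Statement
  /-- unit `vorbis_decode_initial.5`: a segment of `vorbis_decode_initial`, child of the split of `vorbis_decode_initial` -/
  h_vorbis_decode_initial_5 : Vorbis.Spec.vorbis_decode_initial_5.Statement
  /-- unit `vorbis_decode_initial.6`: a segment of `vorbis_decode_initial`, child of the split of `vorbis_decode_initial` -/
  h_vorbis_decode_initial_6 : Vorbis.Spec.vorbis_decode_initial_6.Statement
  /-- unit `vorbis_decode_initial.7`: a segment of `vorbis_decode_initial`, child of the split of `vorbis_decode_initial` -/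
  h_vorbis_decode_initial_7 : Vorbis.Spec.vorbis_decode_initial_7.Statement
  /-- unit `vorbis_decode_initial.8`: a segment of `vorbis_decode_initial`, child of the split of `vorbis_decode_initial` -/
  h_vorbis_decode_initial_8 : Vorbis.Spec.vorbis_decode_initial_8.Statement
  /-- unit `vorbis_decode_initial.9`: a segment of `vorbis_decode_initial`, child of the split of `vorbis_decode_initial` -/
  h_vorbis_decode_initial_9 : Vorbis.Spec.vorbis_decode_initial_9.Statement
  /-- unit `vorbis_decode_packet`: a whole function -/
  h_vorbis_decode_packet : Vorbis.Spec.vorbis_decode_packet.Statement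
  /-- unit `stb_vorbis_get_frame_float.1`: a segment of `stb_vorbis_get_frame_float`, child of the split of `stb_vorbis_get_frame_float` -/
  h_stb_vorbis_get_frame_float_1 : Vorbis.Spec.stb_vorbis_get_frame_float_1.Statement
  /-- unit `stb_vorbis_get_frame_float.2`: a segment of `stb_vorbis_get_frame_float`, child of the split of `stb_vorbis_get_frame_float` -/
  h_stb_vorbis_get_frame_float_2 : Vorbis.Spec.stb_vorbis_get_frame_float_2.Statement
  /-- unit `stb_vorbis_get_frame_float.3`: a segment of `stb_vorbis_get_frame_float`, child of the split of `stb_vorbis_get_frame_float` -/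
  h_stb_vorbis_get_frame_float_3 : Vorbis.Spec.stb_vorbis_get_frame_float_3.Statement
  /-- unit `stb_vorbis_get_frame_float.4`: a segment of `stb_vorbis_get_frame_float`, child of the split of `stb_vorbis_get_frame_float` -/
  h_stb_vorbis_get_frame_float_4 : Vorbis.Spec.stb_vorbis_get_frame_float_4.Statement
  /-- unit `stb_vorbis_get_frame_float.5`: a segment of `stb_vorbis_get_frame_float`, child of the split of `stb_vorbis_get_frame_float` -/
  h_stb_vorbis_get_frame_float_5 : Vorbis.Spec.stb_vorbis_get_frame_float_5.Statement
  /-- unit `stb_vorbis_get_frame_float.6`: a segment of `stb_vorbis_get_frame_float`, child of the split of `stb_vorbis_get_frame_float` -/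
  h_stb_vorbis_get_frame_float_6 : Vorbis.Spec.stb_vorbis_get_frame_float_6.Statement
  /-- unit `range_bad`: a whole function -/
  h_range_bad : Vorbis.Spec.range_bad.Statement
  /-- unit `__asan_storeN_noabort`: a whole function -/
  h_asan_storeN_noabort : Vorbis.Spec.asan_storeN_noabort.Statement
  /-- unit `__asan_load16_noabort`: a whole function -/
  h_asan_load16_noabort : Vorbis.Spec.asan_load16_noabort.Statement
  /-- unit `__asan_store16_noabort`: a whole function -/
  h_asan_store16_noabort : Vorbis.Spec.asan_store16_noabort.Statement
  /-- unit `vorbis_init`: a whole function -/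
  h_vorbis_init : Vorbis.Spec.vorbis_init.Statement
  /-- unit `setup_malloc`: a whole function -/
  h_setup_malloc : Vorbis.Spec.setup_malloc.Statement
  /-- unit `vorbis_alloc`: a whole function -/
  h_vorbis_alloc : Vorbis.Spec.vorbis_alloc.Statement
  /-- unit `vorbis_pump_first_frame`: a whole function -/
  h_vorbis_pump_first_frame : Vorbis.Spec.vorbis_pump_first_frame.Statement
  /-- unit `swap_bytes`: a whole function -/
  h_swap_bytes : Vorbis.Spec.swap_bytes.Statement
  /-- unit `uint32_compare`: a whole function -/
  h_uint32_compare : Vorbis.Spec.uint32_compare.Statement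
  /-- unit `point_compare`: a whole function -/
  h_point_compare : Vorbis.Spec.point_compare.Statement
  /-- unit `sift_down`: a whole function -/
  h_sift_down : Vorbis.Spec.sift_down.Statement
  /-- unit `qsort`: a whole function -/
  h_qsort : Vorbis.Spec.qsort.Statement
  /-- unit `crc32_init`: a whole function -/
  h_crc32_init : Vorbis.Spec.crc32_init.Statement
  /-- unit `compute_accelerated_huffman`: a whole function -/
  h_compute_accelerated_huffman : Vorbis.Spec.compute_accelerated_huffman.Statement
  /-- unit `neighbors`: a whole function -/
  h_neighbors : Vorbis.Spec.neighbors.Statement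
  /-- unit `skip`: a whole function -/
  h_skip : Vorbis.Spec.skip.Statement
  /-- unit `add_entry`: a whole function -/
  h_add_entry : Vorbis.Spec.add_entry.Statement
  /-- unit `compute_codewords.1`: a segment of `compute_codewords`, child of the split of `compute_codewords` -/
  h_compute_codewords_1 : Vorbis.Spec.compute_codewords_1.Statement
  /-- unit `compute_codewords.2`: a segment of `compute_codewords`, child of the split of `compute_codewords` -/
  h_compute_codewords_2 : Vorbis.Spec.compute_codewords_2.Statement
  /-- unit `compute_codewords.3`: a segment of `compute_codewords`, child of the split of `compute_codewords` -/
  h_compute_codewords_3 : Vorbis.Spec.compute_codewords_3.Statement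
  /-- unit `compute_codewords.4`: a segment of `compute_codewords`, child of the split of `compute_codewords` -/
  h_compute_codewords_4 : Vorbis.Spec.compute_codewords_4.Statement
  /-- unit `compute_codewords.5`: a segment of `compute_codewords`, child of the split of `compute_codewords` -/
  h_compute_codewords_5 : Vorbis.Spec.compute_codewords_5.Statement
  /-- unit `compute_codewords.6`: a segment of `compute_codewords`, child of the split of `compute_codewords` -/
  h_compute_codewords_6 : Vorbis.Spec.compute_codewords_6.Statement
  /-- unit `compute_codewords.7`: a segment of `compute_codewords`, child of the split of `compute_codewords` -/
  h_compute_codewords_7 : Vorbis.Spec.compute_codewords_7.Statement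
  /-- unit `compute_codewords.8`: a segment of `compute_codewords`, child of the split of `compute_codewords` -/
  h_compute_codewords_8 : Vorbis.Spec.compute_codewords_8.Statement
  /-- unit `compute_codewords.9`: a segment of `compute_codewords`, child of the split of `compute_codewords` -/
  h_compute_codewords_9 : Vorbis.Spec.compute_codewords_9.Statement
  /-- unit `setup_temp_free`: a whole function (proves `setup_temp_free.weakSpec`) -/
  h_setup_temp_free : Vorbis.Spec.setup_temp_free.Statement
  /-- unit `include_in_sort`: a whole function -/
  h_include_in_sort : Vorbis.Spec.include_in_sort.Statement
  /-- unit `compute_sorted_huffman.1`: a segment of `compute_sorted_huffman` -/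
  h_compute_sorted_huffman_1 : Vorbis.Spec.compute_sorted_huffman_1.Statement
  /-- unit `compute_sorted_huffman.2`: a segment of `compute_sorted_huffman` -/
  h_compute_sorted_huffman_2 : Vorbis.Spec.compute_sorted_huffman_2.Statement
  /-- unit `compute_sorted_huffman.3`: a segment of `compute_sorted_huffman` -/
  h_compute_sorted_huffman_3 : Vorbis.Spec.compute_sorted_huffman_3.Statement
  /-- unit `compute_sorted_huffman.4`: a segment of `compute_sorted_huffman` -/
  h_compute_sorted_huffman_4 : Vorbis.Spec.compute_sorted_huffman_4.Statement
  /-- unit `memcmp`: a whole function -/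
  h_memcmp : Vorbis.Spec.memcmp.Statement
  /-- unit `vorbis_validate`: a whole function -/
  h_vorbis_validate : Vorbis.Spec.vorbis_validate.Statement
  /-- unit `two_to`: a whole function -/
  h_two_to : Vorbis.Spec.two_to.Statement
  /-- unit `ldexp`: a whole function -/
  h_ldexp : Vorbis.Spec.ldexp.Statement
  /-- unit `float32_unpack`: a whole function -/
  h_float32_unpack : Vorbis.Spec.float32_unpack.Statement
  /-- unit `floor`: a whole function -/
  h_floor : Vorbis.Spec.floor.Statement
  /-- unit `exp`: a whole function -/
  h_exp : Vorbis.Spec.exp.Statement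
  /-- unit `log`: a whole function -/
  h_log : Vorbis.Spec.log.Statement
  /-- unit `pow_int`: a whole function -/
  h_pow_int : Vorbis.Spec.pow_int.Statement
  /-- unit `pow`: a whole function -/
  h_pow : Vorbis.Spec.pow.Statement
  /-- unit `lookup1_values`: a whole function -/
  h_lookup1_values : Vorbis.Spec.lookup1_values.Statement
  /-- unit `compute_bitreverse`: a whole function -/
  h_compute_bitreverse : Vorbis.Spec.compute_bitreverse.Statement
  /-- unit `sin_poly`: a whole function -/
  h_sin_poly : Vorbis.Spec.sin_poly.Statement
  /-- unit `cos_poly`: a whole function -/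
  h_cos_poly : Vorbis.Spec.cos_poly.Statement
  /-- unit `sincos_quadrant`: a whole function -/
  h_sincos_quadrant : Vorbis.Spec.sincos_quadrant.Statement
  /-- unit `sin`: a whole function -/
  h_sin : Vorbis.Spec.sin.Statement
  /-- unit `cos`: a whole function -/
  h_cos : Vorbis.Spec.cos.Statement
  /-- unit `compute_twiddle_factors`: a whole function -/
  h_compute_twiddle_factors : Vorbis.Spec.compute_twiddle_factors.Statement
  /-- unit `square`: a whole function -/
  h_square : Vorbis.Spec.square.Statement
  /-- unit `compute_window`: a whole function -/
  h_compute_window : Vorbis.Spec.compute_window.Statement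
  /-- unit `init_blocksize`: a whole function -/
  h_init_blocksize : Vorbis.Spec.init_blocksize.Statement
  /-- unit `get32_packet`: a whole function -/
  h_get32_packet : Vorbis.Spec.get32_packet.Statement
  /-- unit `start_decoder.1`: a segment of `start_decoder` -/
  h_start_decoder_1 : Vorbis.Spec.start_decoder_1.Statement
  /-- unit `start_decoder.2a`: a segment of `start_decoder`, child of the split of `start_decoder.2` -/
  h_start_decoder_2a : Vorbis.Spec.start_decoder_2a.Statement
  /-- unit `start_decoder.2b`: a segment of `start_decoder`, child of the split of `start_decoder.2` -/
  h_start_decoder_2b : Vorbis.Spec.start_decoder_2b.Statement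
  /-- unit `start_decoder.2c`: a segment of `start_decoder`, child of the split of `start_decoder.2` -/
  h_start_decoder_2c : Vorbis.Spec.start_decoder_2c.Statement
  /-- unit `start_decoder.2d`: a segment of `start_decoder`, child of the split of `start_decoder.2` -/
  h_start_decoder_2d : Vorbis.Spec.start_decoder_2d.Statement
  /-- unit `start_decoder.3`: a segment of `start_decoder` -/
  h_start_decoder_3 : Vorbis.Spec.start_decoder_3.Statement
  /-- unit `start_decoder.4`: a segment of `start_decoder` -/
  h_start_decoder_4 : Vorbis.Spec.start_decoder_4.Statement
  /-- unit `start_decoder.5`: a segment of `start_decoder` -/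
  h_start_decoder_5 : Vorbis.Spec.start_decoder_5.Statement
  /-- unit `start_decoder.6`: a segment of `start_decoder` -/
  h_start_decoder_6 : Vorbis.Spec.start_decoder_6.Statement
  /-- unit `start_decoder.7`: a segment of `start_decoder` -/
  h_start_decoder_7 : Vorbis.Spec.start_decoder_7.Statement
  /-- unit `start_decoder.8`: a segment of `start_decoder` -/
  h_start_decoder_8 : Vorbis.Spec.start_decoder_8.Statement
  /-- unit `start_decoder.9a`: a segment of `start_decoder`, child of the split of `start_decoder.9` -/
  h_start_decoder_9a : Vorbis.Spec.start_decoder_9a.Statement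
  /-- unit `start_decoder.9b`: a segment of `start_decoder`, child of the split of `start_decoder.9` -/
  h_start_decoder_9b : Vorbis.Spec.start_decoder_9b.Statement
  /-- unit `start_decoder.9c`: a segment of `start_decoder`, child of the split of `start_decoder.9` -/
  h_start_decoder_9c : Vorbis.Spec.start_decoder_9c.Statement
  /-- unit `start_decoder.9d`: a segment of `start_decoder`, child of the split of `start_decoder.9` -/
  h_start_decoder_9d : Vorbis.Spec.start_decoder_9d.Statement
  /-- unit `start_decoder.9e`: a segment of `start_decoder`, child of the split of `start_decoder.9` -/
  h_start_decoder_9e : Vorbis.Spec.start_decoder_9e.Statement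
  /-- unit `start_decoder.9f`: a segment of `start_decoder`, child of the split of `start_decoder.9` -/
  h_start_decoder_9f : Vorbis.Spec.start_decoder_9f.Statement
  /-- unit `start_decoder.ERR`: a segment of `start_decoder` -/
  h_start_decoder_ERR : Vorbis.Spec.start_decoder_ERR.Statement
  /-- unit `start_decoder.C1`: a segment of `start_decoder` -/
  h_start_decoder_C1 : Vorbis.Spec.start_decoder_C1.Statement
  /-- unit `start_decoder.C2a`: a segment of `start_decoder`, child of the split of `start_decoder.C2` -/
  h_start_decoder_C2a : Vorbis.Spec.start_decoder_C2a.Statement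
  /-- unit `start_decoder.C2b`: a segment of `start_decoder`, child of the split of `start_decoder.C2` -/
  h_start_decoder_C2b : Vorbis.Spec.start_decoder_C2b.Statement
  /-- unit `start_decoder.C2c`: a segment of `start_decoder`, child of the split of `start_decoder.C2` -/
  h_start_decoder_C2c : Vorbis.Spec.start_decoder_C2c.Statement
  /-- unit `start_decoder.C2d`: a segment of `start_decoder`, child of the split of `start_decoder.C2` -/
  h_start_decoder_C2d : Vorbis.Spec.start_decoder_C2d.Statement
  /-- unit `start_decoder.C3a`: a segment of `start_decoder`, child of the split of `start_decoder.C3` -/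
  h_start_decoder_C3a : Vorbis.Spec.start_decoder_C3a.Statement
  /-- unit `start_decoder.C3b`: a segment of `start_decoder`, child of the split of `start_decoder.C3` -/
  h_start_decoder_C3b : Vorbis.Spec.start_decoder_C3b.Statement
  /-- unit `start_decoder.C3c`: a segment of `start_decoder`, child of the split of `start_decoder.C3` -/
  h_start_decoder_C3c : Vorbis.Spec.start_decoder_C3c.Statement
  /-- unit `start_decoder.C4a`: a segment of `start_decoder`, child of the split of `start_decoder.C4` -/
  h_start_decoder_C4a : Vorbis.Spec.start_decoder_C4a.Statement
  /-- unit `start_decoder.C4b`: a segment of `start_decoder`, child of the split of `start_decoder.C4` -/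
  h_start_decoder_C4b : Vorbis.Spec.start_decoder_C4b.Statement
  /-- unit `start_decoder.C4c`: a segment of `start_decoder`, child of the split of `start_decoder.C4` -/
  h_start_decoder_C4c : Vorbis.Spec.start_decoder_C4c.Statement
  /-- unit `start_decoder.C4d`: a segment of `start_decoder`, child of the split of `start_decoder.C4` -/
  h_start_decoder_C4d : Vorbis.Spec.start_decoder_C4d.Statement
  /-- unit `start_decoder.C5a`: a segment of `start_decoder`, child of the split of `start_decoder.C5` -/
  h_start_decoder_C5a : Vorbis.Spec.start_decoder_C5a.Statement
  /-- unit `start_decoder.C5b`: a segment of `start_decoder`, child of the split of `start_decoder.C5` -/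
  h_start_decoder_C5b : Vorbis.Spec.start_decoder_C5b.Statement
  /-- unit `start_decoder.C5c`: a segment of `start_decoder`, child of the split of `start_decoder.C5` -/
  h_start_decoder_C5c : Vorbis.Spec.start_decoder_C5c.Statement
  /-- unit `start_decoder.C5d`: a segment of `start_decoder`, child of the split of `start_decoder.C5` -/
  h_start_decoder_C5d : Vorbis.Spec.start_decoder_C5d.Statement
  /-- unit `start_decoder.C5e`: a segment of `start_decoder`, child of the split of `start_decoder.C5` -/
  h_start_decoder_C5e : Vorbis.Spec.start_decoder_C5e.Statement
  /-- unit `start_decoder.C6a`: a segment of `start_decoder`, child of the split of `start_decoder.C6` -/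
  h_start_decoder_C6a : Vorbis.Spec.start_decoder_C6a.Statement
  /-- unit `start_decoder.C6b`: a segment of `start_decoder`, child of the split of `start_decoder.C6` -/
  h_start_decoder_C6b : Vorbis.Spec.start_decoder_C6b.Statement
  /-- unit `start_decoder.C6c`: a segment of `start_decoder`, child of the split of `start_decoder.C6` -/
  h_start_decoder_C6c : Vorbis.Spec.start_decoder_C6c.Statement
  /-- unit `start_decoder.C6d`: a segment of `start_decoder`, child of the split of `start_decoder.C6` -/
  h_start_decoder_C6d : Vorbis.Spec.start_decoder_C6d.Statement
  /-- unit `start_decoder.C6e`: a segment of `start_decoder`, child of the split of `start_decoder.C6` -/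
  h_start_decoder_C6e : Vorbis.Spec.start_decoder_C6e.Statement
  /-- unit `start_decoder.C7a`: a segment of `start_decoder`, child of the split of `start_decoder.C7` -/
  h_start_decoder_C7a : Vorbis.Spec.start_decoder_C7a.Statement
  /-- unit `start_decoder.C7b`: a segment of `start_decoder`, child of the split of `start_decoder.C7` -/
  h_start_decoder_C7b : Vorbis.Spec.start_decoder_C7b.Statement
  /-- unit `start_decoder.C8a`: a segment of `start_decoder`, child of the split of `start_decoder.C8` -/
  h_start_decoder_C8a : Vorbis.Spec.start_decoder_C8a.Statement
  /-- unit `start_decoder.C8b`: a segment of `start_decoder`, child of the split of `start_decoder.C8` -/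
  h_start_decoder_C8b : Vorbis.Spec.start_decoder_C8b.Statement
  /-- unit `start_decoder.C8c`: a segment of `start_decoder`, child of the split of `start_decoder.C8` -/
  h_start_decoder_C8c : Vorbis.Spec.start_decoder_C8c.Statement
  /-- unit `start_decoder.C8d`: a segment of `start_decoder`, child of the split of `start_decoder.C8` -/
  h_start_decoder_C8d : Vorbis.Spec.start_decoder_C8d.Statement
  /-- unit `start_decoder.C8e`: a segment of `start_decoder`, child of the split of `start_decoder.C8` -/
  h_start_decoder_C8e : Vorbis.Spec.start_decoder_C8e.Statement
  /-- unit `start_decoder.C8f`: a segment of `start_decoder`, child of the split of `start_decoder.C8` -/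
  h_start_decoder_C8f : Vorbis.Spec.start_decoder_C8f.Statement
  /-- unit `start_decoder.C9a`: a segment of `start_decoder`, child of the split of `start_decoder.C9` -/
  h_start_decoder_C9a : Vorbis.Spec.start_decoder_C9a.Statement
  /-- unit `start_decoder.C9b`: a segment of `start_decoder`, child of the split of `start_decoder.C9` -/
  h_start_decoder_C9b : Vorbis.Spec.start_decoder_C9b.Statement
  /-- unit `start_decoder.C9c`: a segment of `start_decoder`, child of the split of `start_decoder.C9` -/
  h_start_decoder_C9c : Vorbis.Spec.start_decoder_C9c.Statement
  /-- unit `start_decoder.C9d`: a segment of `start_decoder`, child of the split of `start_decoder.C9` -/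
  h_start_decoder_C9d : Vorbis.Spec.start_decoder_C9d.Statement
  /-- unit `start_decoder.C10`: a segment of `start_decoder` -/
  h_start_decoder_C10 : Vorbis.Spec.start_decoder_C10.Statement
  /-- unit `start_decoder.C11a`: a segment of `start_decoder`, child of the split of `start_decoder.C11` -/
  h_start_decoder_C11a : Vorbis.Spec.start_decoder_C11a.Statement
  /-- unit `start_decoder.C11b`: a segment of `start_decoder`, child of the split of `start_decoder.C11` -/
  h_start_decoder_C11b : Vorbis.Spec.start_decoder_C11b.Statement
  /-- unit `start_decoder.C11c`: a segment of `start_decoder`, child of the split of `start_decoder.C11` -/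
  h_start_decoder_C11c : Vorbis.Spec.start_decoder_C11c.Statement
  /-- unit `start_decoder.C11d`: a segment of `start_decoder`, child of the split of `start_decoder.C11` -/
  h_start_decoder_C11d : Vorbis.Spec.start_decoder_C11d.Statement
  /-- unit `start_decoder.C11e`: a segment of `start_decoder`, child of the split of `start_decoder.C11` -/
  h_start_decoder_C11e : Vorbis.Spec.start_decoder_C11e.Statement
  /-- unit `start_decoder.C11f`: a segment of `start_decoder`, child of the split of `start_decoder.C11` -/
  h_start_decoder_C11f : Vorbis.Spec.start_decoder_C11f.Statement
  /-- unit `start_decoder.C11g`: a segment of `start_decoder`, child of the split of `start_decoder.C11` -/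
  h_start_decoder_C11g : Vorbis.Spec.start_decoder_C11g.Statement
  /-- unit `start_decoder.C12`: a segment of `start_decoder` -/
  h_start_decoder_C12 : Vorbis.Spec.start_decoder_C12.Statement
  /-- unit `start_decoder.C13a`: a segment of `start_decoder`, child of the split of `start_decoder.C13` -/
  h_start_decoder_C13a : Vorbis.Spec.start_decoder_C13a.Statement
  /-- unit `start_decoder.C13b`: a segment of `start_decoder`, child of the split of `start_decoder.C13` -/
  h_start_decoder_C13b : Vorbis.Spec.start_decoder_C13b.Statement
  /-- unit `start_decoder.C13c`: a segment of `start_decoder`, child of the split of `start_decoder.C13` -/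
  h_start_decoder_C13c : Vorbis.Spec.start_decoder_C13c.Statement
  /-- unit `start_decoder.C13d`: a segment of `start_decoder`, child of the split of `start_decoder.C13` -/
  h_start_decoder_C13d : Vorbis.Spec.start_decoder_C13d.Statement
  /-- unit `start_decoder.C14a`: a segment of `start_decoder`, child of the split of `start_decoder.C14` -/
  h_start_decoder_C14a : Vorbis.Spec.start_decoder_C14a.Statement
  /-- unit `start_decoder.C14b`: a segment of `start_decoder`, child of the split of `start_decoder.C14` -/
  h_start_decoder_C14b : Vorbis.Spec.start_decoder_C14b.Statement
  /-- unit `start_decoder.C14c`: a segment of `start_decoder`, child of the split of `start_decoder.C14` -/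
  h_start_decoder_C14c : Vorbis.Spec.start_decoder_C14c.Statement
  /-- unit `start_decoder.C15`: a segment of `start_decoder` -/
  h_start_decoder_C15 : Vorbis.Spec.start_decoder_C15.Statement
  /-- unit `start_decoder.C16`: a segment of `start_decoder` -/
  h_start_decoder_C16 : Vorbis.Spec.start_decoder_C16.Statement
  /-- unit `start_decoder.F1`: a segment of `start_decoder` -/
  h_start_decoder_F1 : Vorbis.Spec.start_decoder_F1.Statement
  /-- unit `start_decoder.F2a`: a segment of `start_decoder`, child of the split of `start_decoder.F2` -/
  h_start_decoder_F2a : Vorbis.Spec.start_decoder_F2a.Statement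
  /-- unit `start_decoder.F2b`: a segment of `start_decoder`, child of the split of `start_decoder.F2` -/
  h_start_decoder_F2b : Vorbis.Spec.start_decoder_F2b.Statement
  /-- unit `start_decoder.F2c`: a segment of `start_decoder`, child of the split of `start_decoder.F2` -/
  h_start_decoder_F2c : Vorbis.Spec.start_decoder_F2c.Statement
  /-- unit `start_decoder.F2d`: a segment of `start_decoder`, child of the split of `start_decoder.F2` -/
  h_start_decoder_F2d : Vorbis.Spec.start_decoder_F2d.Statement
  /-- unit `start_decoder.F3`: a segment of `start_decoder` -/
  h_start_decoder_F3 : Vorbis.Spec.start_decoder_F3.Statement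
  /-- unit `start_decoder.F4a`: a segment of `start_decoder`, child of the split of `start_decoder.F4` -/
  h_start_decoder_F4a : Vorbis.Spec.start_decoder_F4a.Statement
  /-- unit `start_decoder.F4b`: a segment of `start_decoder`, child of the split of `start_decoder.F4` -/
  h_start_decoder_F4b : Vorbis.Spec.start_decoder_F4b.Statement
  /-- unit `start_decoder.F4c`: a segment of `start_decoder`, child of the split of `start_decoder.F4` -/
  h_start_decoder_F4c : Vorbis.Spec.start_decoder_F4c.Statement
  /-- unit `start_decoder.F4d`: a segment of `start_decoder`, child of the split of `start_decoder.F4` -/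
  h_start_decoder_F4d : Vorbis.Spec.start_decoder_F4d.Statement
  /-- unit `start_decoder.F4e`: a segment of `start_decoder`, child of the split of `start_decoder.F4` -/
  h_start_decoder_F4e : Vorbis.Spec.start_decoder_F4e.Statement
  /-- unit `start_decoder.F5a`: a segment of `start_decoder`, child of the split of `start_decoder.F5` -/
  h_start_decoder_F5a : Vorbis.Spec.start_decoder_F5a.Statement
  /-- unit `start_decoder.F5b`: a segment of `start_decoder`, child of the split of `start_decoder.F5` -/
  h_start_decoder_F5b : Vorbis.Spec.start_decoder_F5b.Statement
  /-- unit `start_decoder.F5c`: a segment of `start_decoder`, child of the split of `start_decoder.F5` -/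
  h_start_decoder_F5c : Vorbis.Spec.start_decoder_F5c.Statement
  /-- unit `start_decoder.F5d`: a segment of `start_decoder`, child of the split of `start_decoder.F5` -/
  h_start_decoder_F5d : Vorbis.Spec.start_decoder_F5d.Statement
  /-- unit `start_decoder.F5e`: a segment of `start_decoder`, child of the split of `start_decoder.F5` -/
  h_start_decoder_F5e : Vorbis.Spec.start_decoder_F5e.Statement
  /-- unit `start_decoder.F5f`: a segment of `start_decoder`, child of the split of `start_decoder.F5` -/
  h_start_decoder_F5f : Vorbis.Spec.start_decoder_F5f.Statement
  /-- unit `start_decoder.F6a`: a segment of `start_decoder`, child of the split of `start_decoder.F6` -/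
  h_start_decoder_F6a : Vorbis.Spec.start_decoder_F6a.Statement
  /-- unit `start_decoder.F6b`: a segment of `start_decoder`, child of the split of `start_decoder.F6` -/
  h_start_decoder_F6b : Vorbis.Spec.start_decoder_F6b.Statement
  /-- unit `start_decoder.F6c`: a segment of `start_decoder`, child of the split of `start_decoder.F6` -/
  h_start_decoder_F6c : Vorbis.Spec.start_decoder_F6c.Statement
  /-- unit `start_decoder.F6d`: a segment of `start_decoder`, child of the split of `start_decoder.F6` -/
  h_start_decoder_F6d : Vorbis.Spec.start_decoder_F6d.Statement
  /-- unit `start_decoder.F7`: a segment of `start_decoder` -/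
  h_start_decoder_F7 : Vorbis.Spec.start_decoder_F7.Statement
  /-- unit `start_decoder.R1a`: a segment of `start_decoder`, child of the split of `start_decoder.R1` -/
  h_start_decoder_R1a : Vorbis.Spec.start_decoder_R1a.Statement
  /-- unit `start_decoder.R1b`: a segment of `start_decoder`, child of the split of `start_decoder.R1` -/
  h_start_decoder_R1b : Vorbis.Spec.start_decoder_R1b.Statement
  /-- unit `start_decoder.R1c`: a segment of `start_decoder`, child of the split of `start_decoder.R1` -/
  h_start_decoder_R1c : Vorbis.Spec.start_decoder_R1c.Statement
  /-- unit `start_decoder.R1d`: a segment of `start_decoder`, child of the split of `start_decoder.R1` -/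
  h_start_decoder_R1d : Vorbis.Spec.start_decoder_R1d.Statement
  /-- unit `start_decoder.R2`: a segment of `start_decoder` -/
  h_start_decoder_R2 : Vorbis.Spec.start_decoder_R2.Statement
  /-- unit `start_decoder.R3`: a segment of `start_decoder` -/
  h_start_decoder_R3 : Vorbis.Spec.start_decoder_R3.Statement
  /-- unit `start_decoder.R4`: a segment of `start_decoder` -/
  h_start_decoder_R4 : Vorbis.Spec.start_decoder_R4.Statement
  /-- unit `start_decoder.R5`: a segment of `start_decoder` -/
  h_start_decoder_R5 : Vorbis.Spec.start_decoder_R5.Statement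
  /-- unit `start_decoder.R6`: a segment of `start_decoder` -/
  h_start_decoder_R6 : Vorbis.Spec.start_decoder_R6.Statement
  /-- unit `start_decoder.R7a`: a segment of `start_decoder`, child of the split of `start_decoder.R7` -/
  h_start_decoder_R7a : Vorbis.Spec.start_decoder_R7a.Statement
  /-- unit `start_decoder.R7b`: a segment of `start_decoder`, child of the split of `start_decoder.R7` -/
  h_start_decoder_R7b : Vorbis.Spec.start_decoder_R7b.Statement
  /-- unit `start_decoder.R7c`: a segment of `start_decoder`, child of the split of `start_decoder.R7` -/
  h_start_decoder_R7c : Vorbis.Spec.start_decoder_R7c.Statement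
  /-- unit `start_decoder.R8`: a segment of `start_decoder` -/
  h_start_decoder_R8 : Vorbis.Spec.start_decoder_R8.Statement
  /-- unit `start_decoder.R9`: a segment of `start_decoder` -/
  h_start_decoder_R9 : Vorbis.Spec.start_decoder_R9.Statement
  /-- unit `start_decoder.R10`: a segment of `start_decoder` -/
  h_start_decoder_R10 : Vorbis.Spec.start_decoder_R10.Statement
  /-- unit `start_decoder.R11`: a segment of `start_decoder` -/
  h_start_decoder_R11 : Vorbis.Spec.start_decoder_R11.Statement
  /-- unit `start_decoder.R12a`: a segment of `start_decoder`, child of the split of `start_decoder.R12` -/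
  h_start_decoder_R12a : Vorbis.Spec.start_decoder_R12a.Statement
  /-- unit `start_decoder.R12b`: a segment of `start_decoder`, child of the split of `start_decoder.R12` -/
  h_start_decoder_R12b : Vorbis.Spec.start_decoder_R12b.Statement
  /-- unit `start_decoder.R12c`: a segment of `start_decoder`, child of the split of `start_decoder.R12` -/
  h_start_decoder_R12c : Vorbis.Spec.start_decoder_R12c.Statement
  /-- unit `start_decoder.R12d`: a segment of `start_decoder`, child of the split of `start_decoder.R12` -/
  h_start_decoder_R12d : Vorbis.Spec.start_decoder_R12d.Statement
  /-- unit `start_decoder.R13`: a segment of `start_decoder` -/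
  h_start_decoder_R13 : Vorbis.Spec.start_decoder_R13.Statement
  /-- unit `start_decoder.R14`: a segment of `start_decoder` -/
  h_start_decoder_R14 : Vorbis.Spec.start_decoder_R14.Statement
  /-- unit `start_decoder.R15`: a segment of `start_decoder` -/
  h_start_decoder_R15 : Vorbis.Spec.start_decoder_R15.Statement
  /-- unit `start_decoder.R16`: a segment of `start_decoder` -/
  h_start_decoder_R16 : Vorbis.Spec.start_decoder_R16.Statement
  /-- unit `start_decoder.R17`: a segment of `start_decoder` -/
  h_start_decoder_R17 : Vorbis.Spec.start_decoder_R17.Statement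
  /-- unit `start_decoder.R18`: a segment of `start_decoder` -/
  h_start_decoder_R18 : Vorbis.Spec.start_decoder_R18.Statement
  /-- unit `start_decoder.R19`: a segment of `start_decoder` -/
  h_start_decoder_R19 : Vorbis.Spec.start_decoder_R19.Statement
  /-- unit `stb_vorbis_open_memory`: a whole function -/
  h_stb_vorbis_open_memory : Vorbis.Spec.stb_vorbis_open_memory.Statement
  /-- unit `decode_all.1`: a segment of `decode_all`, child of the split of `decode_all` -/
  h_decode_all_1 : Vorbis.Spec.decode_all_1.Statement
  /-- unit `decode_all.2`: a segment of `decode_all`, child of the split of `decode_all` -/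
  h_decode_all_2 : Vorbis.Spec.decode_all_2.Statement
  /-- unit `decode_all.3`: a segment of `decode_all`, child of the split of `decode_all` -/
  h_decode_all_3 : Vorbis.Spec.decode_all_3.Statement
  /-- unit `decode_all.4`: a segment of `decode_all`, child of the split of `decode_all` -/
  h_decode_all_4 : Vorbis.Spec.decode_all_4.Statement
  /-- unit `decode_all.5`: a segment of `decode_all`, child of the split of `decode_all` -/
  h_decode_all_5 : Vorbis.Spec.decode_all_5.Statement
  /-- unit `decode_all.6`: a segment of `decode_all`, child of the split of `decode_all` -/
  h_decode_all_6 : Vorbis.Spec.decode_all_6.Statement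
  /-- unit `decode_all.7`: a segment of `decode_all`, child of the split of `decode_all` -/
  h_decode_all_7 : Vorbis.Spec.decode_all_7.Statement
  /-- unit `_start_vorbis`: the stub (hand-written statement) -/
  h_start_vorbis : Vorbis.Spec.start_vorbis.Statement

namespace Assembly

/-! ### 1. The split parents: the children's statements give the parent's -/

/-- The statement of the split unit `vorbis_finish_frame`, from its children's (`vorbis_finish_frame.1`, `vorbis_finish_frame.2`, `vorbis_finish_frame.3`, `vorbis_finish_frame.4`, `vorbis_finish_frame.5`, `vorbis_finish_frame.COMPOSITION`). -/
theorem stmt_vorbis_finish_frame (L : Final.Leaves) : Vorbis.Spec.vorbis_finish_frame.Statement :=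
  Vorbis.Spec.Splits.vorbis_finish_frame
    L.h_vorbis_finish_frame_1
    L.h_vorbis_finish_frame_2
    L.h_vorbis_finish_frame_3
    L.h_vorbis_finish_frame_4
    L.h_vorbis_finish_frame_5
    Vorbis.Spec.Worked.vorbis_finish_frame_COMPOSITION_ok

/-- The statement of the split unit `inverse_mdct.7`, from its children's (`inverse_mdct.7a`, `inverse_mdct.7b`). -/
theorem stmt_inverse_mdct_7 (L : Final.Leaves) : Vorbis.Spec.inverse_mdct_7.Statement :=
  Vorbis.Spec.Splits.inverse_mdct_7
    L.h_inverse_mdct_7a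
    L.h_inverse_mdct_7b

/-- The statement of the split unit `codebook_decode_deinterleave_repeat.2`, from its children's (`codebook_decode_deinterleave_repeat.2a`, `codebook_decode_deinterleave_repeat.2b`, `codebook_decode_deinterleave_repeat.2c`, `codebook_decode_deinterleave_repeat.2d`). -/
theorem stmt_codebook_decode_deinterleave_repeat_2 (L : Final.Leaves) : Vorbis.Spec.codebook_decode_deinterleave_repeat_2.Statement :=
  Vorbis.Spec.Splits.codebook_decode_deinterleave_repeat_2
    L.h_codebook_decode_deinterleave_repeat_2a
    L.h_codebook_decode_deinterleave_repeat_2b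
    L.h_codebook_decode_deinterleave_repeat_2c
    L.h_codebook_decode_deinterleave_repeat_2d

/-- The statement of the split unit `decode_residue.1`, from its children's (`decode_residue.1a`, `decode_residue.1b`, `decode_residue.1c`, `decode_residue.1d`). -/
theorem stmt_decode_residue_1 (L : Final.Leaves) : Vorbis.Spec.decode_residue_1.Statement :=
  Vorbis.Spec.Splits.decode_residue_1
    L.h_decode_residue_1a
    L.h_decode_residue_1b
    L.h_decode_residue_1c
    L.h_decode_residue_1d

/-- The statement of the split unit `decode_residue.4`, from its children's (`decode_residue.4a`, `decode_residue.4b`). -/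
theorem stmt_decode_residue_4 (L : Final.Leaves) : Vorbis.Spec.decode_residue_4.Statement :=
  Vorbis.Spec.Splits.decode_residue_4
    L.h_decode_residue_4a
    L.h_decode_residue_4b

/-- The statement of the split unit `decode_residue.6b`, from its children's (`decode_residue.6ba`, `decode_residue.6bb`). -/
theorem stmt_decode_residue_6b (L : Final.Leaves) : Vorbis.Spec.decode_residue_6b.Statement :=
  Vorbis.Spec.Splits.decode_residue_6b
    L.h_decode_residue_6ba
    L.h_decode_residue_6bb

/-- The statement of the split unit `decode_residue.6`, from its children's (`decode_residue.6a`, `decode_residue.6b`). -/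
theorem stmt_decode_residue_6 (L : Final.Leaves) : Vorbis.Spec.decode_residue_6.Statement :=
  Vorbis.Spec.Splits.decode_residue_6
    L.h_decode_residue_6a
    (stmt_decode_residue_6b L)

/-- The statement of the split unit `decode_residue.7`, from its children's (`decode_residue.7a`, `decode_residue.7b`, `decode_residue.7c`). -/
theorem stmt_decode_residue_7 (L : Final.Leaves) : Vorbis.Spec.decode_residue_7.Statement :=
  Vorbis.Spec.Splits.decode_residue_7
    L.h_decode_residue_7a
    L.h_decode_residue_7b
    L.h_decode_residue_7c

/-- The statement of the split unit `vorbis_decode_packet_rest.1`, from its children's (`vorbis_decode_packet_rest.1a`, `vorbis_decode_packet_rest.1b`). -/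
theorem stmt_vorbis_decode_packet_rest_1 (L : Final.Leaves) : Vorbis.Spec.vorbis_decode_packet_rest_1.Statement :=
  Vorbis.Spec.Splits.vorbis_decode_packet_rest_1
    L.h_vorbis_decode_packet_rest_1a
    L.h_vorbis_decode_packet_rest_1b

/-- The statement of the split unit `vorbis_decode_packet_rest.2`, from its children's (`vorbis_decode_packet_rest.2a`, `vorbis_decode_packet_rest.2b`, `vorbis_decode_packet_rest.2c`, `vorbis_decode_packet_rest.2d`). -/
theorem stmt_vorbis_decode_packet_rest_2 (L : Final.Leaves) : Vorbis.Spec.vorbis_decode_packet_rest_2.Statement :=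
  Vorbis.Spec.Splits.vorbis_decode_packet_rest_2
    L.h_vorbis_decode_packet_rest_2a
    L.h_vorbis_decode_packet_rest_2b
    L.h_vorbis_decode_packet_rest_2c
    L.h_vorbis_decode_packet_rest_2d

/-- The statement of the split unit `vorbis_decode_packet_rest.3`, from its children's (`vorbis_decode_packet_rest.3a`, `vorbis_decode_packet_rest.3b`, `vorbis_decode_packet_rest.3c`). -/
theorem stmt_vorbis_decode_packet_rest_3 (L : Final.Leaves) : Vorbis.Spec.vorbis_decode_packet_rest_3.Statement :=
  Vorbis.Spec.Splits.vorbis_decode_packet_rest_3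
    L.h_vorbis_decode_packet_rest_3a
    L.h_vorbis_decode_packet_rest_3b
    L.h_vorbis_decode_packet_rest_3c

/-- The statement of the split unit `vorbis_decode_packet_rest.4`, from its children's (`vorbis_decode_packet_rest.4a`, `vorbis_decode_packet_rest.4b`, `vorbis_decode_packet_rest.4c`, `vorbis_decode_packet_rest.4d`, `vorbis_decode_packet_rest.4e`). -/
theorem stmt_vorbis_decode_packet_rest_4 (L : Final.Leaves) : Vorbis.Spec.vorbis_decode_packet_rest_4.Statement :=
  Vorbis.Spec.Splits.vorbis_decode_packet_rest_4
    L.h_vorbis_decode_packet_rest_4a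
    L.h_vorbis_decode_packet_rest_4b
    L.h_vorbis_decode_packet_rest_4c
    L.h_vorbis_decode_packet_rest_4d
    L.h_vorbis_decode_packet_rest_4e

/-- The statement of the split unit `vorbis_decode_packet_rest.5`, from its children's (`vorbis_decode_packet_rest.5a`, `vorbis_decode_packet_rest.5b`, `vorbis_decode_packet_rest.5c`). -/
theorem stmt_vorbis_decode_packet_rest_5 (L : Final.Leaves) : Vorbis.Spec.vorbis_decode_packet_rest_5.Statement :=
  Vorbis.Spec.Splits.vorbis_decode_packet_rest_5
    L.h_vorbis_decode_packet_rest_5a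
    L.h_vorbis_decode_packet_rest_5b
    L.h_vorbis_decode_packet_rest_5c

/-- The statement of the split unit `vorbis_decode_initial`, from its children's (`vorbis_decode_initial.1`, `vorbis_decode_initial.2`, `vorbis_decode_initial.3`, `vorbis_decode_initial.4`, `vorbis_decode_initial.5`, `vorbis_decode_initial.6`, `vorbis_decode_initial.7`, `vorbis_decode_initial.8`, `vorbis_decode_initial.9`, `vorbis_decode_initial.COMPOSITION`). -/
theorem stmt_vorbis_decode_initial (L : Final.Leaves) : Vorbis.Spec.vorbis_decode_initial.Statement :=
  Vorbis.Spec.Splits.vorbis_decode_initial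
    L.h_vorbis_decode_initial_1
    L.h_vorbis_decode_initial_2
    L.h_vorbis_decode_initial_3
    L.h_vorbis_decode_initial_4
    L.h_vorbis_decode_initial_5
    L.h_vorbis_decode_initial_6
    L.h_vorbis_decode_initial_7
    L.h_vorbis_decode_initial_8
    L.h_vorbis_decode_initial_9
    Vorbis.Spec.Worked.vorbis_decode_initial_COMPOSITION_ok

/-- The statement of the split unit `stb_vorbis_get_frame_float`, from its children's (`stb_vorbis_get_frame_float.1`, `stb_vorbis_get_frame_float.2`, `stb_vorbis_get_frame_float.3`, `stb_vorbis_get_frame_float.4`, `stb_vorbis_get_frame_float.5`, `stb_vorbis_get_frame_float.6`, `stb_vorbis_get_frame_float.COMPOSITION`). -/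
theorem stmt_stb_vorbis_get_frame_float (L : Final.Leaves) : Vorbis.Spec.stb_vorbis_get_frame_float.Statement :=
  Vorbis.Spec.Splits.stb_vorbis_get_frame_float
    L.h_stb_vorbis_get_frame_float_1
    L.h_stb_vorbis_get_frame_float_2
    L.h_stb_vorbis_get_frame_float_3
    L.h_stb_vorbis_get_frame_float_4
    L.h_stb_vorbis_get_frame_float_5
    L.h_stb_vorbis_get_frame_float_6
    Vorbis.Spec.Worked.stb_vorbis_get_frame_float_COMPOSITION_ok

/-- The statement of the split unit `compute_codewords`, from its children's (`compute_codewords.1`, `compute_codewords.2`, `compute_codewords.3`, `compute_codewords.4`, `compute_codewords.5`, `compute_codewords.6`, `compute_codewords.7`, `compute_codewords.8`, `compute_codewords.9`, `compute_codewords.COMPOSITION`). -/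
theorem stmt_compute_codewords (L : Final.Leaves) : Vorbis.Spec.compute_codewords.Statement :=
  Vorbis.Spec.Splits.compute_codewords
    L.h_compute_codewords_1
    L.h_compute_codewords_2
    L.h_compute_codewords_3
    L.h_compute_codewords_4
    L.h_compute_codewords_5
    L.h_compute_codewords_6
    L.h_compute_codewords_7
    L.h_compute_codewords_8
    L.h_compute_codewords_9
    Vorbis.Spec.Worked.compute_codewords_COMPOSITION_ok

/-- The statement of the split unit `start_decoder.2`, from its children's (`start_decoder.2a`, `start_decoder.2b`, `start_decoder.2c`, `start_decoder.2d`). -/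
theorem stmt_start_decoder_2 (L : Final.Leaves) : Vorbis.Spec.start_decoder_2.Statement :=
  Vorbis.Spec.Splits.start_decoder_2
    L.h_start_decoder_2a
    L.h_start_decoder_2b
    L.h_start_decoder_2c
    L.h_start_decoder_2d

/-- The statement of the split unit `start_decoder.9`, from its children's (`start_decoder.9a`, `start_decoder.9b`, `start_decoder.9c`, `start_decoder.9d`, `start_decoder.9e`, `start_decoder.9f`). -/
theorem stmt_start_decoder_9 (L : Final.Leaves) : Vorbis.Spec.start_decoder_9.Statement :=
  Vorbis.Spec.Splits.start_decoder_9
    L.h_start_decoder_9a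
    L.h_start_decoder_9b
    L.h_start_decoder_9c
    L.h_start_decoder_9d
    L.h_start_decoder_9e
    L.h_start_decoder_9f

/-- The statement of the split unit `start_decoder.C2`, from its children's (`start_decoder.C2a`, `start_decoder.C2b`, `start_decoder.C2c`, `start_decoder.C2d`). -/
theorem stmt_start_decoder_C2 (L : Final.Leaves) : Vorbis.Spec.start_decoder_C2.Statement :=
  Vorbis.Spec.Splits.start_decoder_C2
    L.h_start_decoder_C2a
    L.h_start_decoder_C2b
    L.h_start_decoder_C2c
    L.h_start_decoder_C2d

/-- The statement of the split unit `start_decoder.C3`, from its children's (`start_decoder.C3a`, `start_decoder.C3b`, `start_decoder.C3c`). -/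
theorem stmt_start_decoder_C3 (L : Final.Leaves) : Vorbis.Spec.start_decoder_C3.Statement :=
  Vorbis.Spec.Splits.start_decoder_C3
    L.h_start_decoder_C3a
    L.h_start_decoder_C3b
    L.h_start_decoder_C3c

/-- The statement of the split unit `start_decoder.C4`, from its children's (`start_decoder.C4a`, `start_decoder.C4b`, `start_decoder.C4c`, `start_decoder.C4d`). -/
theorem stmt_start_decoder_C4 (L : Final.Leaves) : Vorbis.Spec.start_decoder_C4.Statement :=
  Vorbis.Spec.Splits.start_decoder_C4
    L.h_start_decoder_C4a
    L.h_start_decoder_C4b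
    L.h_start_decoder_C4c
    L.h_start_decoder_C4d

/-- The statement of the split unit `start_decoder.C5`, from its children's (`start_decoder.C5a`, `start_decoder.C5b`, `start_decoder.C5c`, `start_decoder.C5d`, `start_decoder.C5e`). -/
theorem stmt_start_decoder_C5 (L : Final.Leaves) : Vorbis.Spec.start_decoder_C5.Statement :=
  Vorbis.Spec.Splits.start_decoder_C5
    L.h_start_decoder_C5a
    L.h_start_decoder_C5b
    L.h_start_decoder_C5c
    L.h_start_decoder_C5d
    L.h_start_decoder_C5e

/-- The statement of the split unit `start_decoder.C6`, from its children's (`start_decoder.C6a`, `start_decoder.C6b`, `start_decoder.C6c`, `start_decoder.C6d`, `start_decoder.C6e`). -/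
theorem stmt_start_decoder_C6 (L : Final.Leaves) : Vorbis.Spec.start_decoder_C6.Statement :=
  Vorbis.Spec.Splits.start_decoder_C6
    L.h_start_decoder_C6a
    L.h_start_decoder_C6b
    L.h_start_decoder_C6c
    L.h_start_decoder_C6d
    L.h_start_decoder_C6e

/-- The statement of the split unit `start_decoder.C7`, from its children's (`start_decoder.C7a`, `start_decoder.C7b`). -/
theorem stmt_start_decoder_C7 (L : Final.Leaves) : Vorbis.Spec.start_decoder_C7.Statement :=
  Vorbis.Spec.Splits.start_decoder_C7
    L.h_start_decoder_C7a
    L.h_start_decoder_C7b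

/-- The statement of the split unit `start_decoder.C8`, from its children's (`start_decoder.C8a`, `start_decoder.C8b`, `start_decoder.C8c`, `start_decoder.C8d`, `start_decoder.C8e`, `start_decoder.C8f`). -/
theorem stmt_start_decoder_C8 (L : Final.Leaves) : Vorbis.Spec.start_decoder_C8.Statement :=
  Vorbis.Spec.Splits.start_decoder_C8
    L.h_start_decoder_C8a
    L.h_start_decoder_C8b
    L.h_start_decoder_C8c
    L.h_start_decoder_C8d
    L.h_start_decoder_C8e
    L.h_start_decoder_C8f

/-- The statement of the split unit `start_decoder.C9`, from its children's (`start_decoder.C9a`, `start_decoder.C9b`, `start_decoder.C9c`, `start_decoder.C9d`). -/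
theorem stmt_start_decoder_C9 (L : Final.Leaves) : Vorbis.Spec.start_decoder_C9.Statement :=
  Vorbis.Spec.Splits.start_decoder_C9
    L.h_start_decoder_C9a
    L.h_start_decoder_C9b
    L.h_start_decoder_C9c
    L.h_start_decoder_C9d

/-- The statement of the split unit `start_decoder.C11`, from its children's (`start_decoder.C11a`, `start_decoder.C11b`, `start_decoder.C11c`, `start_decoder.C11d`, `start_decoder.C11e`, `start_decoder.C11f`, `start_decoder.C11g`). -/
theorem stmt_start_decoder_C11 (L : Final.Leaves) : Vorbis.Spec.start_decoder_C11.Statement :=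
  Vorbis.Spec.Splits.start_decoder_C11
    L.h_start_decoder_C11a
    L.h_start_decoder_C11b
    L.h_start_decoder_C11c
    L.h_start_decoder_C11d
    L.h_start_decoder_C11e
    L.h_start_decoder_C11f
    L.h_start_decoder_C11g

/-- The statement of the split unit `start_decoder.C13`, from its children's (`start_decoder.C13a`, `start_decoder.C13b`, `start_decoder.C13c`, `start_decoder.C13d`). -/
theorem stmt_start_decoder_C13 (L : Final.Leaves) : Vorbis.Spec.start_decoder_C13.Statement :=
  Vorbis.Spec.Splits.start_decoder_C13
    L.h_start_decoder_C13a
    L.h_start_decoder_C13b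
    L.h_start_decoder_C13c
    L.h_start_decoder_C13d

/-- The statement of the split unit `start_decoder.C14`, from its children's (`start_decoder.C14a`, `start_decoder.C14b`, `start_decoder.C14c`). -/
theorem stmt_start_decoder_C14 (L : Final.Leaves) : Vorbis.Spec.start_decoder_C14.Statement :=
  Vorbis.Spec.Splits.start_decoder_C14
    L.h_start_decoder_C14a
    L.h_start_decoder_C14b
    L.h_start_decoder_C14c

/-- The statement of the split unit `start_decoder.F2`, from its children's (`start_decoder.F2a`, `start_decoder.F2b`, `start_decoder.F2c`, `start_decoder.F2d`). -/
theorem stmt_start_decoder_F2 (L : Final.Leaves) : Vorbis.Spec.start_decoder_F2.Statement :=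
  Vorbis.Spec.Splits.start_decoder_F2
    L.h_start_decoder_F2a
    L.h_start_decoder_F2b
    L.h_start_decoder_F2c
    L.h_start_decoder_F2d

/-- The statement of the split unit `start_decoder.F4`, from its children's (`start_decoder.F4a`, `start_decoder.F4b`, `start_decoder.F4c`, `start_decoder.F4d`, `start_decoder.F4e`). -/
theorem stmt_start_decoder_F4 (L : Final.Leaves) : Vorbis.Spec.start_decoder_F4.Statement :=
  Vorbis.Spec.Splits.start_decoder_F4
    L.h_start_decoder_F4a
    L.h_start_decoder_F4b
    L.h_start_decoder_F4c
    L.h_start_decoder_F4d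
    L.h_start_decoder_F4e

/-- The statement of the split unit `start_decoder.F5`, from its children's (`start_decoder.F5a`, `start_decoder.F5b`, `start_decoder.F5c`, `start_decoder.F5d`, `start_decoder.F5e`, `start_decoder.F5f`). -/
theorem stmt_start_decoder_F5 (L : Final.Leaves) : Vorbis.Spec.start_decoder_F5.Statement :=
  Vorbis.Spec.Splits.start_decoder_F5
    L.h_start_decoder_F5a
    L.h_start_decoder_F5b
    L.h_start_decoder_F5c
    L.h_start_decoder_F5d
    L.h_start_decoder_F5e
    L.h_start_decoder_F5f

/-- The statement of the split unit `start_decoder.F6`, from its children's (`start_decoder.F6a`, `start_decoder.F6b`, `start_decoder.F6c`, `start_decoder.F6d`). -/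
theorem stmt_start_decoder_F6 (L : Final.Leaves) : Vorbis.Spec.start_decoder_F6.Statement :=
  Vorbis.Spec.Splits.start_decoder_F6
    L.h_start_decoder_F6a
    L.h_start_decoder_F6b
    L.h_start_decoder_F6c
    L.h_start_decoder_F6d

/-- The statement of the split unit `start_decoder.R1`, from its children's (`start_decoder.R1a`, `start_decoder.R1b`, `start_decoder.R1c`, `start_decoder.R1d`). -/
theorem stmt_start_decoder_R1 (L : Final.Leaves) : Vorbis.Spec.start_decoder_R1.Statement :=
  Vorbis.Spec.Splits.start_decoder_R1
    L.h_start_decoder_R1a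
    L.h_start_decoder_R1b
    L.h_start_decoder_R1c
    L.h_start_decoder_R1d

/-- The statement of the split unit `start_decoder.R7`, from its children's (`start_decoder.R7a`, `start_decoder.R7b`, `start_decoder.R7c`). -/
theorem stmt_start_decoder_R7 (L : Final.Leaves) : Vorbis.Spec.start_decoder_R7.Statement :=
  Vorbis.Spec.Splits.start_decoder_R7
    L.h_start_decoder_R7a
    L.h_start_decoder_R7b
    L.h_start_decoder_R7c

/-- The statement of the split unit `start_decoder.R12`, from its children's (`start_decoder.R12a`, `start_decoder.R12b`, `start_decoder.R12c`, `start_decoder.R12d`). -/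
theorem stmt_start_decoder_R12 (L : Final.Leaves) : Vorbis.Spec.start_decoder_R12.Statement :=
  Vorbis.Spec.Splits.start_decoder_R12
    L.h_start_decoder_R12a
    L.h_start_decoder_R12b
    L.h_start_decoder_R12c
    L.h_start_decoder_R12d

/-- The statement of the split unit `decode_all`, from its children's (`decode_all.1`, `decode_all.2`, `decode_all.3`, `decode_all.4`, `decode_all.5`, `decode_all.6`, `decode_all.7`, `decode_all.COMPOSITION`). -/
theorem stmt_decode_all (L : Final.Leaves) : Vorbis.Spec.decode_all.Statement :=
  Vorbis.Spec.Splits.decode_all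
    L.h_decode_all_1
    L.h_decode_all_2
    L.h_decode_all_3
    L.h_decode_all_4
    L.h_decode_all_5
    L.h_decode_all_6
    L.h_decode_all_7
    Vorbis.Spec.Worked.decode_all_COMPOSITION_ok

/-! ### 2. Bottom-up along the dependency graph: the conclusion of every top-level unit -/

/-- **The contract of `__asan_register_globals`**, from the unit `__asan_register_globals`. -/
theorem ctr_asan_register_globals (L : Final.Leaves) (Lay : Layout) (hLay : Lay.hi = 0x1000000) (μ : Microarch) (hμ : UserX.MicroOK μ) (u₀ : State)
    (hcode : AllCode Lay u₀) :
    Calls Lay μ Vorbis.WayInv (Vorbis.conv u₀) Vorbis.L.__asan_register_globals.entry (Asan.registerGlobalsSpec Vorbis.Spec.rt) :=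
  L.h_asan_register_globals Lay hLay μ hμ u₀ hcode.asan_register_globals

/-- **The contract of `_sub_I_65535_1`**, from the unit `_sub_I_65535_1`. -/
theorem ctr_sub_I_65535_1 (L : Final.Leaves) (Lay : Layout) (hLay : Lay.hi = 0x1000000) (μ : Microarch) (hμ : UserX.MicroOK μ) (u₀ : State)
    (hcode : AllCode Lay u₀) :
    Calls Lay μ Vorbis.WayInv (Vorbis.conv u₀) Vorbis.L._sub_I_65535_1.entry (Asan.ctorSpec Vorbis.Spec.rt) :=
  L.h_sub_I_65535_1 Lay hLay μ hμ u₀ hcode.sub_I_65535_1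
    (ctr_asan_register_globals L Lay hLay μ hμ u₀ hcode)

/-- **The contract of `run_ctors`**, from the unit `run_ctors`. -/
theorem ctr_run_ctors (L : Final.Leaves) (Lay : Layout) (hLay : Lay.hi = 0x1000000) (μ : Microarch) (hμ : UserX.MicroOK μ) (u₀ : State)
    (hcode : AllCode Lay u₀) :
    Calls Lay μ Vorbis.WayInv (Vorbis.conv u₀) Vorbis.L.run_ctors.entry (Asan.runCtorsSpec Vorbis.Spec.rt) :=
  L.h_run_ctors Lay hLay μ hμ u₀ hcode.run_ctors
    (ctr_sub_I_65535_1 L Lay hLay μ hμ u₀ hcode)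

/-- **The contract of `__asan_load4_noabort`**, from the unit `__asan_load4_noabort`. -/
theorem ctr_asan_load4_noabort (L : Final.Leaves) (Lay : Layout) (hLay : Lay.hi = 0x1000000) (μ : Microarch) (hμ : UserX.MicroOK μ) (u₀ : State)
    (hcode : AllCode Lay u₀) :
    Asan.SmallCheck Lay μ Vorbis.WayInv (Vorbis.CodeOK u₀) [.rax, .rcx, .rdx] 4 Vorbis.L.__asan_load4_noabort.entry :=
  L.h_asan_load4_noabort Lay hLay μ hμ u₀ hcode.asan_load4_noabort

/-- **The contract of `__asan_store4_noabort`**, from the unit `__asan_store4_noabort`. -/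
theorem ctr_asan_store4_noabort (L : Final.Leaves) (Lay : Layout) (hLay : Lay.hi = 0x1000000) (μ : Microarch) (hμ : UserX.MicroOK μ) (u₀ : State)
    (hcode : AllCode Lay u₀) :
    Asan.SmallCheck Lay μ Vorbis.WayInv (Vorbis.CodeOK u₀) [.rax, .rcx, .rdx] 4 Vorbis.L.__asan_store4_noabort.entry :=
  L.h_asan_store4_noabort Lay hLay μ hμ u₀ hcode.asan_store4_noabort

/-- **The contract of `__asan_load8_noabort`**, from the unit `__asan_load8_noabort`. -/
theorem ctr_asan_load8_noabort (L : Final.Leaves) (Lay : Layout) (hLay : Lay.hi = 0x1000000) (μ : Microarch) (hμ : UserX.MicroOK μ) (u₀ : State)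
    (hcode : AllCode Lay u₀) :
    Asan.SmallCheck Lay μ Vorbis.WayInv (Vorbis.CodeOK u₀) [.rax, .rcx, .rdx] 8 Vorbis.L.__asan_load8_noabort.entry :=
  L.h_asan_load8_noabort Lay hLay μ hμ u₀ hcode.asan_load8_noabort

/-- **The contract of `copy_frame`**, from the unit `copy_frame`. -/
theorem ctr_copy_frame (L : Final.Leaves) (Lay : Layout) (hLay : Lay.hi = 0x1000000) (μ : Microarch) (hμ : UserX.MicroOK μ) (u₀ : State)
    (hcode : AllCode Lay u₀) :
    ∀ (others : List Obj) (frames : List (Nat × FrameLayout)), Calls Lay μ Vorbis.WayInv (Vorbis.conv u₀) Vorbis.L.copy_frame.entry (Vorbis.Spec.copy_frame.spec others frames) :=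
  L.h_copy_frame Lay hLay μ hμ u₀ hcode.copy_frame
    (ctr_asan_load8_noabort L Lay hLay μ hμ u₀ hcode)
    (ctr_asan_load4_noabort L Lay hLay μ hμ u₀ hcode)
    (ctr_asan_store4_noabort L Lay hLay μ hμ u₀ hcode)

/-- **The contract of `put_header`**, from the unit `put_header`. -/
theorem ctr_put_header (L : Final.Leaves) (Lay : Layout) (hLay : Lay.hi = 0x1000000) (μ : Microarch) (hμ : UserX.MicroOK μ) (u₀ : State)
    (hcode : AllCode Lay u₀) :
    ∀ (others : List Obj) (frames : List (Nat × FrameLayout)), Calls Lay μ Vorbis.WayInv (Vorbis.conv u₀) Vorbis.L.put_header.entry (Vorbis.Spec.put_header.spec others frames) :=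
  L.h_put_header Lay hLay μ hμ u₀ hcode.put_header
    (ctr_asan_store4_noabort L Lay hLay μ hμ u₀ hcode)

/-- **The contract of `free`**, from the unit `free`. -/
theorem ctr_free (L : Final.Leaves) (Lay : Layout) (hLay : Lay.hi = 0x1000000) (μ : Microarch) (hμ : UserX.MicroOK μ) (u₀ : State)
    (hcode : AllCode Lay u₀) :
    ∀ (others : List Obj) (frames : List (Nat × FrameLayout)), Calls Lay μ Vorbis.WayInv (Vorbis.conv u₀) Vorbis.L.free.entry (Vorbis.Spec.free.spec others frames) :=
  L.h_free Lay hLay μ hμ u₀ hcode.free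

/-- **The contract of `setup_free`**, from the unit `setup_free`. -/
theorem ctr_setup_free (L : Final.Leaves) (Lay : Layout) (hLay : Lay.hi = 0x1000000) (μ : Microarch) (hμ : UserX.MicroOK μ) (u₀ : State)
    (hcode : AllCode Lay u₀) :
    ∀ (others : List Obj) (frames : List (Nat × FrameLayout)), Calls Lay μ Vorbis.WayInv (Vorbis.conv u₀) Vorbis.L.setup_free.entry (Vorbis.Spec.setup_free.spec others frames) :=
  L.h_setup_free Lay hLay μ hμ u₀ hcode.setup_free
    (ctr_asan_load8_noabort L Lay hLay μ hμ u₀ hcode)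
    (ctr_free L Lay hLay μ hμ u₀ hcode)

/-- **The contract of `__asan_load1_noabort`**, from the unit `__asan_load1_noabort`. -/
theorem ctr_asan_load1_noabort (L : Final.Leaves) (Lay : Layout) (hLay : Lay.hi = 0x1000000) (μ : Microarch) (hμ : UserX.MicroOK μ) (u₀ : State)
    (hcode : AllCode Lay u₀) :
    Asan.SmallCheck Lay μ Vorbis.WayInv (Vorbis.CodeOK u₀) [.rax, .rdx] 1 Vorbis.L.__asan_load1_noabort.entry :=
  L.h_asan_load1_noabort Lay hLay μ hμ u₀ hcode.asan_load1_noabort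

/-- Segment `vorbis_deinit.1` of `vorbis_deinit`: its claim, from the unit's statement. -/
theorem seg_vorbis_deinit_1 (L : Final.Leaves) (Lay : Layout) (hLay : Lay.hi = 0x1000000) (μ : Microarch) (hμ : UserX.MicroOK μ) (u₀ : State)
    (hcode : AllCode Lay u₀) :
    Vorbis.Spec.vorbis_deinit.Seg1 Lay μ u₀ :=
  L.h_vorbis_deinit_1 Lay hLay μ hμ u₀ hcode.vorbis_deinit
    (ctr_asan_load8_noabort L Lay hLay μ hμ u₀ hcode)
    (ctr_setup_free L Lay hLay μ hμ u₀ hcode)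
    (ctr_asan_load4_noabort L Lay hLay μ hμ u₀ hcode)
    (ctr_asan_load1_noabort L Lay hLay μ hμ u₀ hcode)

/-- Segment `vorbis_deinit.2` of `vorbis_deinit`: its claim, from the unit's statement. -/
theorem seg_vorbis_deinit_2 (L : Final.Leaves) (Lay : Layout) (hLay : Lay.hi = 0x1000000) (μ : Microarch) (hμ : UserX.MicroOK μ) (u₀ : State)
    (hcode : AllCode Lay u₀) :
    Vorbis.Spec.vorbis_deinit.Seg2 Lay μ u₀ :=
  L.h_vorbis_deinit_2 Lay hLay μ hμ u₀ hcode.vorbis_deinit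
    (ctr_asan_load8_noabort L Lay hLay μ hμ u₀ hcode)
    (ctr_setup_free L Lay hLay μ hμ u₀ hcode)
    (ctr_asan_load4_noabort L Lay hLay μ hμ u₀ hcode)

/-- Segment `vorbis_deinit.3` of `vorbis_deinit`: its claim, from the unit's statement. -/
theorem seg_vorbis_deinit_3 (L : Final.Leaves) (Lay : Layout) (hLay : Lay.hi = 0x1000000) (μ : Microarch) (hμ : UserX.MicroOK μ) (u₀ : State)
    (hcode : AllCode Lay u₀) :
    Vorbis.Spec.vorbis_deinit.Seg3 Lay μ u₀ :=
  L.h_vorbis_deinit_3 Lay hLay μ hμ u₀ hcode.vorbis_deinit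
    (ctr_asan_load8_noabort L Lay hLay μ hμ u₀ hcode)
    (ctr_setup_free L Lay hLay μ hμ u₀ hcode)
    (ctr_asan_load4_noabort L Lay hLay μ hμ u₀ hcode)

/-- Segment `vorbis_deinit.4` of `vorbis_deinit`: its claim, from the unit's statement. -/
theorem seg_vorbis_deinit_4 (L : Final.Leaves) (Lay : Layout) (hLay : Lay.hi = 0x1000000) (μ : Microarch) (hμ : UserX.MicroOK μ) (u₀ : State)
    (hcode : AllCode Lay u₀) :
    Vorbis.Spec.vorbis_deinit.Seg4 Lay μ u₀ :=
  L.h_vorbis_deinit_4 Lay hLay μ hμ u₀ hcode.vorbis_deinit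

/-- **The contract of `vorbis_deinit`**, from the composition of its segments (`vorbis_deinit.COMPOSITION`). -/
theorem ctr_vorbis_deinit (L : Final.Leaves) (Lay : Layout) (hLay : Lay.hi = 0x1000000) (μ : Microarch) (hμ : UserX.MicroOK μ) (u₀ : State)
    (hcode : AllCode Lay u₀) :
    ∀ (others : List Obj) (frames : List (Nat × FrameLayout)) (Blk : Block → Prop), Calls Lay μ Vorbis.WayInv (Vorbis.conv u₀) Vorbis.L.vorbis_deinit.entry (Vorbis.Spec.vorbis_deinit.spec others frames Blk) :=
  Vorbis.Spec.Worked.vorbis_deinit_COMPOSITION_ok Lay hLay μ hμ u₀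
    (seg_vorbis_deinit_1 L Lay hLay μ hμ u₀ hcode)
    (seg_vorbis_deinit_2 L Lay hLay μ hμ u₀ hcode)
    (seg_vorbis_deinit_3 L Lay hLay μ hμ u₀ hcode)
    (seg_vorbis_deinit_4 L Lay hLay μ hμ u₀ hcode)

/-- **The contract of `stb_vorbis_close`**, from the unit `stb_vorbis_close`. -/
theorem ctr_stb_vorbis_close (L : Final.Leaves) (Lay : Layout) (hLay : Lay.hi = 0x1000000) (μ : Microarch) (hμ : UserX.MicroOK μ) (u₀ : State)
    (hcode : AllCode Lay u₀) :
    ∀ (others : List Obj) (frames : List (Nat × FrameLayout)) (Blk : Block → Prop), Calls Lay μ Vorbis.WayInv (Vorbis.conv u₀) Vorbis.L.stb_vorbis_close.entry (Vorbis.Spec.stb_vorbis_close.spec others frames Blk) :=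
  L.h_stb_vorbis_close Lay hLay μ hμ u₀ hcode.stb_vorbis_close
    (ctr_vorbis_deinit L Lay hLay μ hμ u₀ hcode)
    (ctr_setup_free L Lay hLay μ hμ u₀ hcode)

/-- **The contract of `stb_vorbis_get_error`**, from the unit `stb_vorbis_get_error`. -/
theorem ctr_stb_vorbis_get_error (L : Final.Leaves) (Lay : Layout) (hLay : Lay.hi = 0x1000000) (μ : Microarch) (hμ : UserX.MicroOK μ) (u₀ : State)
    (hcode : AllCode Lay u₀) :
    ∀ (others : List Obj) (frames : List (Nat × FrameLayout)), Calls Lay μ Vorbis.WayInv (Vorbis.conv u₀) Vorbis.L.stb_vorbis_get_error.entry (Vorbis.Spec.stb_vorbis_get_error.spec others frames) :=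
  L.h_stb_vorbis_get_error Lay hLay μ hμ u₀ hcode.stb_vorbis_get_error
    (ctr_asan_load4_noabort L Lay hLay μ hμ u₀ hcode)

/-- **The contract of `__asan_store8_noabort`**, from the unit `__asan_store8_noabort`. -/
theorem ctr_asan_store8_noabort (L : Final.Leaves) (Lay : Layout) (hLay : Lay.hi = 0x1000000) (μ : Microarch) (hμ : UserX.MicroOK μ) (u₀ : State)
    (hcode : AllCode Lay u₀) :
    Asan.SmallCheck Lay μ Vorbis.WayInv (Vorbis.CodeOK u₀) [.rax, .rcx, .rdx] 8 Vorbis.L.__asan_store8_noabort.entry :=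
  L.h_asan_store8_noabort Lay hLay μ hμ u₀ hcode.asan_store8_noabort

/-- **The contract of `get_window`**, from the unit `get_window`. -/
theorem ctr_get_window (L : Final.Leaves) (Lay : Layout) (hLay : Lay.hi = 0x1000000) (μ : Microarch) (hμ : UserX.MicroOK μ) (u₀ : State)
    (hcode : AllCode Lay u₀) :
    ∀ (others : List Obj) (frames : List (Nat × FrameLayout)), Calls Lay μ Vorbis.WayInv (Vorbis.conv u₀) Vorbis.L.get_window.entry (Vorbis.Spec.get_window.spec others frames) :=
  L.h_get_window Lay hLay μ hμ u₀ hcode.get_window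
    (ctr_asan_load4_noabort L Lay hLay μ hμ u₀ hcode)
    (ctr_asan_load8_noabort L Lay hLay μ hμ u₀ hcode)

/-- **The contract of `vorbis_finish_frame`**, from the unit `vorbis_finish_frame`. -/
theorem ctr_vorbis_finish_frame (L : Final.Leaves) (Lay : Layout) (hLay : Lay.hi = 0x1000000) (μ : Microarch) (hμ : UserX.MicroOK μ) (u₀ : State)
    (hcode : AllCode Lay u₀) :
    ∀ (others : List Obj) (frames : List (Nat × FrameLayout)) (len : Nat) (A : Arena) (stored room : Int) (ysz : Nat → Nat), Calls Lay μ Vorbis.WayInv (Vorbis.conv u₀) Vorbis.L.vorbis_finish_frame.entry (Vorbis.Spec.vorbis_finish_frame.spec others frames len A stored room ysz) :=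
  (stmt_vorbis_finish_frame L) Lay hLay μ hμ u₀ hcode.vorbis_finish_frame
    (ctr_asan_load4_noabort L Lay hLay μ hμ u₀ hcode)
    (ctr_get_window L Lay hLay μ hμ u₀ hcode)
    (ctr_asan_load8_noabort L Lay hLay μ hμ u₀ hcode)
    (ctr_asan_store4_noabort L Lay hLay μ hμ u₀ hcode)

/-- **The contract of `__asan_store1_noabort`**, from the unit `__asan_store1_noabort`. -/
theorem ctr_asan_store1_noabort (L : Final.Leaves) (Lay : Layout) (hLay : Lay.hi = 0x1000000) (μ : Microarch) (hμ : UserX.MicroOK μ) (u₀ : State)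
    (hcode : AllCode Lay u₀) :
    Asan.SmallCheck Lay μ Vorbis.WayInv (Vorbis.CodeOK u₀) [.rax, .rdx] 1 Vorbis.L.__asan_store1_noabort.entry :=
  L.h_asan_store1_noabort Lay hLay μ hμ u₀ hcode.asan_store1_noabort

/-- **The contract of `__asan_load2_noabort`**, from the unit `__asan_load2_noabort`. -/
theorem ctr_asan_load2_noabort (L : Final.Leaves) (Lay : Layout) (hLay : Lay.hi = 0x1000000) (μ : Microarch) (hμ : UserX.MicroOK μ) (u₀ : State)
    (hcode : AllCode Lay u₀) :
    Asan.SmallCheck Lay μ Vorbis.WayInv (Vorbis.CodeOK u₀) [.rax, .rcx, .rdx] 2 Vorbis.L.__asan_load2_noabort.entry :=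
  L.h_asan_load2_noabort Lay hLay μ hμ u₀ hcode.asan_load2_noabort

/-- **The contract of `__asan_store2_noabort`**, from the unit `__asan_store2_noabort`. -/
theorem ctr_asan_store2_noabort (L : Final.Leaves) (Lay : Layout) (hLay : Lay.hi = 0x1000000) (μ : Microarch) (hμ : UserX.MicroOK μ) (u₀ : State)
    (hcode : AllCode Lay u₀) :
    Asan.SmallCheck Lay μ Vorbis.WayInv (Vorbis.CodeOK u₀) [.rax, .rcx, .rdx] 2 Vorbis.L.__asan_store2_noabort.entry :=
  L.h_asan_store2_noabort Lay hLay μ hμ u₀ hcode.asan_store2_noabort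

/-- **The contract of `memcpy`**, from the unit `memcpy`. -/
theorem ctr_memcpy (L : Final.Leaves) (Lay : Layout) (hLay : Lay.hi = 0x1000000) (μ : Microarch) (hμ : UserX.MicroOK μ) (u₀ : State)
    (hcode : AllCode Lay u₀) :
    ∀ (others : List Obj) (frames : List (Nat × FrameLayout)), Calls Lay μ Vorbis.WayInv (Vorbis.conv u₀) Vorbis.L.memcpy.entry (Vorbis.Spec.memcpy.spec others frames) :=
  L.h_memcpy Lay hLay μ hμ u₀ hcode.memcpy
    (ctr_asan_load1_noabort L Lay hLay μ hμ u₀ hcode)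
    (ctr_asan_store1_noabort L Lay hLay μ hμ u₀ hcode)

/-- **The contract of `memset`**, from the unit `memset`. -/
theorem ctr_memset (L : Final.Leaves) (Lay : Layout) (hLay : Lay.hi = 0x1000000) (μ : Microarch) (hμ : UserX.MicroOK μ) (u₀ : State)
    (hcode : AllCode Lay u₀) :
    ∀ (others : List Obj) (frames : List (Nat × FrameLayout)), Calls Lay μ Vorbis.WayInv (Vorbis.conv u₀) Vorbis.L.memset.entry (Vorbis.Spec.memset.spec others frames) :=
  L.h_memset Lay hLay μ hμ u₀ hcode.memset
    (ctr_asan_store1_noabort L Lay hLay μ hμ u₀ hcode)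

/-- **The contract of `error`**, from the unit `error`. -/
theorem ctr_error (L : Final.Leaves) (Lay : Layout) (hLay : Lay.hi = 0x1000000) (μ : Microarch) (hμ : UserX.MicroOK μ) (u₀ : State)
    (hcode : AllCode Lay u₀) :
    ∀ (others : List Obj) (frames : List (Nat × FrameLayout)), Calls Lay μ Vorbis.WayInv (Vorbis.conv u₀) Vorbis.L.error.entry (Vorbis.Spec.error.spec others frames) :=
  L.h_error Lay hLay μ hμ u₀ hcode.error
    (ctr_asan_store4_noabort L Lay hLay μ hμ u₀ hcode)

/-- **The contract of `ilog`**, from the unit `ilog`. -/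
theorem ctr_ilog (L : Final.Leaves) (Lay : Layout) (hLay : Lay.hi = 0x1000000) (μ : Microarch) (hμ : UserX.MicroOK μ) (u₀ : State)
    (hcode : AllCode Lay u₀) :
    ∀ (others : List Obj) (frames : List (Nat × FrameLayout)), Calls Lay μ Vorbis.WayInv (Vorbis.conv u₀) Vorbis.L.ilog.entry (Vorbis.Spec.ilog.spec others frames) :=
  L.h_ilog Lay hLay μ hμ u₀ hcode.ilog
    (ctr_asan_load1_noabort L Lay hLay μ hμ u₀ hcode)

/-- **The contract of `abs`**, from the unit `abs`. -/
theorem ctr_abs (L : Final.Leaves) (Lay : Layout) (hLay : Lay.hi = 0x1000000) (μ : Microarch) (hμ : UserX.MicroOK μ) (u₀ : State)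
    (hcode : AllCode Lay u₀) :
    ∀ (others : List Obj) (frames : List (Nat × FrameLayout)), Calls Lay μ Vorbis.WayInv (Vorbis.conv u₀) Vorbis.L.abs.entry (Vorbis.Spec.abs.spec others frames) :=
  L.h_abs Lay hLay μ hμ u₀ hcode.abs

/-- **The contract of `predict_point`**, from the unit `predict_point`. -/
theorem ctr_predict_point (L : Final.Leaves) (Lay : Layout) (hLay : Lay.hi = 0x1000000) (μ : Microarch) (hμ : UserX.MicroOK μ) (u₀ : State)
    (hcode : AllCode Lay u₀) :
    ∀ (others : List Obj) (frames : List (Nat × FrameLayout)), Calls Lay μ Vorbis.WayInv (Vorbis.conv u₀) Vorbis.L.predict_point.entry (Vorbis.Spec.predict_point.spec others frames) :=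
  L.h_predict_point Lay hLay μ hμ u₀ hcode.predict_point
    (ctr_abs L Lay hLay μ hμ u₀ hcode)

/-- **The contract of `draw_line`**, from the unit `draw_line`. -/
theorem ctr_draw_line (L : Final.Leaves) (Lay : Layout) (hLay : Lay.hi = 0x1000000) (μ : Microarch) (hμ : UserX.MicroOK μ) (u₀ : State)
    (hcode : AllCode Lay u₀) :
    ∀ (others : List Obj) (frames : List (Nat × FrameLayout)), Calls Lay μ Vorbis.WayInv (Vorbis.conv u₀) Vorbis.L.draw_line.entry (Vorbis.Spec.draw_line.spec others frames) :=
  L.h_draw_line Lay hLay μ hμ u₀ hcode.draw_line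
    (ctr_abs L Lay hLay μ hμ u₀ hcode)
    (ctr_asan_load4_noabort L Lay hLay μ hμ u₀ hcode)

/-- **The contract of `do_floor`**, from the unit `do_floor`. -/
theorem ctr_do_floor (L : Final.Leaves) (Lay : Layout) (hLay : Lay.hi = 0x1000000) (μ : Microarch) (hμ : UserX.MicroOK μ) (u₀ : State)
    (hcode : AllCode Lay u₀) :
    ∀ (others : List Obj) (frames : List (Nat × FrameLayout)) (Blk : Block → Prop) (mi : Nat), Calls Lay μ Vorbis.WayInv (Vorbis.conv u₀) Vorbis.L.do_floor.entry (Vorbis.Spec.do_floor.spec others frames Blk mi) :=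
  L.h_do_floor Lay hLay μ hμ u₀ hcode.do_floor
    (ctr_asan_load8_noabort L Lay hLay μ hμ u₀ hcode)
    (ctr_asan_load1_noabort L Lay hLay μ hμ u₀ hcode)
    (ctr_asan_load2_noabort L Lay hLay μ hμ u₀ hcode)
    (ctr_error L Lay hLay μ hμ u₀ hcode)
    (ctr_draw_line L Lay hLay μ hμ u₀ hcode)
    (ctr_asan_load4_noabort L Lay hLay μ hμ u₀ hcode)

/-- Segment `imdct_step3_iter0_loop.1` of `imdct_step3_iter0_loop`: its claim, from the unit's statement. -/
theorem seg_imdct_step3_iter0_loop_1 (L : Final.Leaves) (Lay : Layout) (hLay : Lay.hi = 0x1000000) (μ : Microarch) (hμ : UserX.MicroOK μ) (u₀ : State)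
    (hcode : AllCode Lay u₀) :
    Vorbis.Spec.imdct_step3_iter0_loop.Seg1 Lay μ u₀ :=
  L.h_imdct_step3_iter0_loop_1 Lay hLay μ hμ u₀ hcode.imdct_step3_iter0_loop

/-- Segment `imdct_step3_iter0_loop.2` of `imdct_step3_iter0_loop`: its claim, from the unit's statement. -/
theorem seg_imdct_step3_iter0_loop_2 (L : Final.Leaves) (Lay : Layout) (hLay : Lay.hi = 0x1000000) (μ : Microarch) (hμ : UserX.MicroOK μ) (u₀ : State)
    (hcode : AllCode Lay u₀) :
    Vorbis.Spec.imdct_step3_iter0_loop.Seg2 Lay μ u₀ :=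
  L.h_imdct_step3_iter0_loop_2 Lay hLay μ hμ u₀ hcode.imdct_step3_iter0_loop
    (ctr_asan_load4_noabort L Lay hLay μ hμ u₀ hcode)

/-- Segment `imdct_step3_iter0_loop.3` of `imdct_step3_iter0_loop`: its claim, from the unit's statement. -/
theorem seg_imdct_step3_iter0_loop_3 (L : Final.Leaves) (Lay : Layout) (hLay : Lay.hi = 0x1000000) (μ : Microarch) (hμ : UserX.MicroOK μ) (u₀ : State)
    (hcode : AllCode Lay u₀) :
    Vorbis.Spec.imdct_step3_iter0_loop.Seg3 Lay μ u₀ :=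
  L.h_imdct_step3_iter0_loop_3 Lay hLay μ hμ u₀ hcode.imdct_step3_iter0_loop
    (ctr_asan_load4_noabort L Lay hLay μ hμ u₀ hcode)

/-- Segment `imdct_step3_iter0_loop.4` of `imdct_step3_iter0_loop`: its claim, from the unit's statement. -/
theorem seg_imdct_step3_iter0_loop_4 (L : Final.Leaves) (Lay : Layout) (hLay : Lay.hi = 0x1000000) (μ : Microarch) (hμ : UserX.MicroOK μ) (u₀ : State)
    (hcode : AllCode Lay u₀) :
    Vorbis.Spec.imdct_step3_iter0_loop.Seg4 Lay μ u₀ :=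
  L.h_imdct_step3_iter0_loop_4 Lay hLay μ hμ u₀ hcode.imdct_step3_iter0_loop

/-- **The contract of `imdct_step3_iter0_loop`**, from the composition of its segments (`imdct_step3_iter0_loop.COMPOSITION`). -/
theorem ctr_imdct_step3_iter0_loop (L : Final.Leaves) (Lay : Layout) (hLay : Lay.hi = 0x1000000) (μ : Microarch) (hμ : UserX.MicroOK μ) (u₀ : State)
    (hcode : AllCode Lay u₀) :
    ∀ (others : List Obj) (frames : List (Nat × FrameLayout)) (len i0 koff : Nat), Calls Lay μ Vorbis.WayInv (Vorbis.conv u₀) Vorbis.L.imdct_step3_iter0_loop.entry (Vorbis.Spec.imdct_step3_iter0_loop.spec others frames len i0 koff) :=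
  Vorbis.Spec.Worked.imdct_step3_iter0_loop_COMPOSITION_ok Lay hLay μ hμ u₀
    (seg_imdct_step3_iter0_loop_1 L Lay hLay μ hμ u₀ hcode)
    (seg_imdct_step3_iter0_loop_2 L Lay hLay μ hμ u₀ hcode)
    (seg_imdct_step3_iter0_loop_3 L Lay hLay μ hμ u₀ hcode)
    (seg_imdct_step3_iter0_loop_4 L Lay hLay μ hμ u₀ hcode)

/-- Segment `imdct_step3_inner_r_loop.1` of `imdct_step3_inner_r_loop`: its claim, from the unit's statement. -/
theorem seg_imdct_step3_inner_r_loop_1 (L : Final.Leaves) (Lay : Layout) (hLay : Lay.hi = 0x1000000) (μ : Microarch) (hμ : UserX.MicroOK μ) (u₀ : State)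
    (hcode : AllCode Lay u₀) :
    Vorbis.Spec.imdct_step3_inner_r_loop.Seg1 Lay μ u₀ :=
  L.h_imdct_step3_inner_r_loop_1 Lay hLay μ hμ u₀ hcode.imdct_step3_inner_r_loop

/-- Segment `imdct_step3_inner_r_loop.2` of `imdct_step3_inner_r_loop`: its claim, from the unit's statement. -/
theorem seg_imdct_step3_inner_r_loop_2 (L : Final.Leaves) (Lay : Layout) (hLay : Lay.hi = 0x1000000) (μ : Microarch) (hμ : UserX.MicroOK μ) (u₀ : State)
    (hcode : AllCode Lay u₀) :
    Vorbis.Spec.imdct_step3_inner_r_loop.Seg2 Lay μ u₀ :=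
  L.h_imdct_step3_inner_r_loop_2 Lay hLay μ hμ u₀ hcode.imdct_step3_inner_r_loop
    (ctr_asan_load4_noabort L Lay hLay μ hμ u₀ hcode)

/-- Segment `imdct_step3_inner_r_loop.3` of `imdct_step3_inner_r_loop`: its claim, from the unit's statement. -/
theorem seg_imdct_step3_inner_r_loop_3 (L : Final.Leaves) (Lay : Layout) (hLay : Lay.hi = 0x1000000) (μ : Microarch) (hμ : UserX.MicroOK μ) (u₀ : State)
    (hcode : AllCode Lay u₀) :
    Vorbis.Spec.imdct_step3_inner_r_loop.Seg3 Lay μ u₀ :=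
  L.h_imdct_step3_inner_r_loop_3 Lay hLay μ hμ u₀ hcode.imdct_step3_inner_r_loop
    (ctr_asan_load4_noabort L Lay hLay μ hμ u₀ hcode)

/-- Segment `imdct_step3_inner_r_loop.4` of `imdct_step3_inner_r_loop`: its claim, from the unit's statement. -/
theorem seg_imdct_step3_inner_r_loop_4 (L : Final.Leaves) (Lay : Layout) (hLay : Lay.hi = 0x1000000) (μ : Microarch) (hμ : UserX.MicroOK μ) (u₀ : State)
    (hcode : AllCode Lay u₀) :
    Vorbis.Spec.imdct_step3_inner_r_loop.Seg4 Lay μ u₀ :=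
  L.h_imdct_step3_inner_r_loop_4 Lay hLay μ hμ u₀ hcode.imdct_step3_inner_r_loop

/-- **The contract of `imdct_step3_inner_r_loop`**, from the composition of its segments (`imdct_step3_inner_r_loop.COMPOSITION`). -/
theorem ctr_imdct_step3_inner_r_loop (L : Final.Leaves) (Lay : Layout) (hLay : Lay.hi = 0x1000000) (μ : Microarch) (hμ : UserX.MicroOK μ) (u₀ : State)
    (hcode : AllCode Lay u₀) :
    ∀ (others : List Obj) (frames : List (Nat × FrameLayout)) (len i0 koff k1 : Nat), Calls Lay μ Vorbis.WayInv (Vorbis.conv u₀) Vorbis.L.imdct_step3_inner_r_loop.entry (Vorbis.Spec.imdct_step3_inner_r_loop.spec others frames len i0 koff k1) :=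
  Vorbis.Spec.Worked.imdct_step3_inner_r_loop_COMPOSITION_ok Lay hLay μ hμ u₀
    (seg_imdct_step3_inner_r_loop_1 L Lay hLay μ hμ u₀ hcode)
    (seg_imdct_step3_inner_r_loop_2 L Lay hLay μ hμ u₀ hcode)
    (seg_imdct_step3_inner_r_loop_3 L Lay hLay μ hμ u₀ hcode)
    (seg_imdct_step3_inner_r_loop_4 L Lay hLay μ hμ u₀ hcode)

/-- Segment `imdct_step3_inner_s_loop.1` of `imdct_step3_inner_s_loop`: its claim, from the unit's statement. -/
theorem seg_imdct_step3_inner_s_loop_1 (L : Final.Leaves) (Lay : Layout) (hLay : Lay.hi = 0x1000000) (μ : Microarch) (hμ : UserX.MicroOK μ) (u₀ : State)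
    (hcode : AllCode Lay u₀) :
    Vorbis.Spec.imdct_step3_inner_s_loop.Seg1 Lay μ u₀ :=
  L.h_imdct_step3_inner_s_loop_1 Lay hLay μ hμ u₀ hcode.imdct_step3_inner_s_loop
    (ctr_asan_load4_noabort L Lay hLay μ hμ u₀ hcode)

/-- Segment `imdct_step3_inner_s_loop.2` of `imdct_step3_inner_s_loop`: its claim, from the unit's statement. -/
theorem seg_imdct_step3_inner_s_loop_2 (L : Final.Leaves) (Lay : Layout) (hLay : Lay.hi = 0x1000000) (μ : Microarch) (hμ : UserX.MicroOK μ) (u₀ : State)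
    (hcode : AllCode Lay u₀) :
    Vorbis.Spec.imdct_step3_inner_s_loop.Seg2 Lay μ u₀ :=
  L.h_imdct_step3_inner_s_loop_2 Lay hLay μ hμ u₀ hcode.imdct_step3_inner_s_loop
    (ctr_asan_load4_noabort L Lay hLay μ hμ u₀ hcode)

/-- Segment `imdct_step3_inner_s_loop.3` of `imdct_step3_inner_s_loop`: its claim, from the unit's statement. -/
theorem seg_imdct_step3_inner_s_loop_3 (L : Final.Leaves) (Lay : Layout) (hLay : Lay.hi = 0x1000000) (μ : Microarch) (hμ : UserX.MicroOK μ) (u₀ : State)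
    (hcode : AllCode Lay u₀) :
    Vorbis.Spec.imdct_step3_inner_s_loop.Seg3 Lay μ u₀ :=
  L.h_imdct_step3_inner_s_loop_3 Lay hLay μ hμ u₀ hcode.imdct_step3_inner_s_loop

/-- **The contract of `imdct_step3_inner_s_loop`**, from the composition of its segments (`imdct_step3_inner_s_loop.COMPOSITION`). -/
theorem ctr_imdct_step3_inner_s_loop (L : Final.Leaves) (Lay : Layout) (hLay : Lay.hi = 0x1000000) (μ : Microarch) (hμ : UserX.MicroOK μ) (u₀ : State)
    (hcode : AllCode Lay u₀) :
    ∀ (others : List Obj) (frames : List (Nat × FrameLayout)) (len i0 koff k0 aoff : Nat), Calls Lay μ Vorbis.WayInv (Vorbis.conv u₀) Vorbis.L.imdct_step3_inner_s_loop.entry (Vorbis.Spec.imdct_step3_inner_s_loop.spec others frames len i0 koff k0 aoff) :=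
  Vorbis.Spec.Worked.imdct_step3_inner_s_loop_COMPOSITION_ok Lay hLay μ hμ u₀
    (seg_imdct_step3_inner_s_loop_1 L Lay hLay μ hμ u₀ hcode)
    (seg_imdct_step3_inner_s_loop_2 L Lay hLay μ hμ u₀ hcode)
    (seg_imdct_step3_inner_s_loop_3 L Lay hLay μ hμ u₀ hcode)

/-- **The contract of `iter_54`**, from the unit `iter_54`. -/
theorem ctr_iter_54 (L : Final.Leaves) (Lay : Layout) (hLay : Lay.hi = 0x1000000) (μ : Microarch) (hμ : UserX.MicroOK μ) (u₀ : State)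
    (hcode : AllCode Lay u₀) :
    ∀ (others : List Obj) (frames : List (Nat × FrameLayout)), Calls Lay μ Vorbis.WayInv (Vorbis.conv u₀) Vorbis.L.iter_54.entry (Vorbis.Spec.iter_54.spec others frames) :=
  L.h_iter_54 Lay hLay μ hμ u₀ hcode.iter_54
    (ctr_asan_load4_noabort L Lay hLay μ hμ u₀ hcode)

/-- Segment `imdct_step3_inner_s_loop_ld654.1` of `imdct_step3_inner_s_loop_ld654`: its claim, from the unit's statement. -/
theorem seg_imdct_step3_inner_s_loop_ld654_1 (L : Final.Leaves) (Lay : Layout) (hLay : Lay.hi = 0x1000000) (μ : Microarch) (hμ : UserX.MicroOK μ) (u₀ : State)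
    (hcode : AllCode Lay u₀) :
    Vorbis.Spec.imdct_step3_inner_s_loop_ld654.Seg1 Lay μ u₀ :=
  L.h_imdct_step3_inner_s_loop_ld654_1 Lay hLay μ hμ u₀ hcode.imdct_step3_inner_s_loop_ld654
    (ctr_asan_load4_noabort L Lay hLay μ hμ u₀ hcode)

/-- Segment `imdct_step3_inner_s_loop_ld654.2` of `imdct_step3_inner_s_loop_ld654`: its claim, from the unit's statement. -/
theorem seg_imdct_step3_inner_s_loop_ld654_2 (L : Final.Leaves) (Lay : Layout) (hLay : Lay.hi = 0x1000000) (μ : Microarch) (hμ : UserX.MicroOK μ) (u₀ : State)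
    (hcode : AllCode Lay u₀) :
    Vorbis.Spec.imdct_step3_inner_s_loop_ld654.Seg2 Lay μ u₀ :=
  L.h_imdct_step3_inner_s_loop_ld654_2 Lay hLay μ hμ u₀ hcode.imdct_step3_inner_s_loop_ld654
    (ctr_asan_load4_noabort L Lay hLay μ hμ u₀ hcode)
    (ctr_iter_54 L Lay hLay μ hμ u₀ hcode)

/-- Segment `imdct_step3_inner_s_loop_ld654.3` of `imdct_step3_inner_s_loop_ld654`: its claim, from the unit's statement. -/
theorem seg_imdct_step3_inner_s_loop_ld654_3 (L : Final.Leaves) (Lay : Layout) (hLay : Lay.hi = 0x1000000) (μ : Microarch) (hμ : UserX.MicroOK μ) (u₀ : State)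
    (hcode : AllCode Lay u₀) :
    Vorbis.Spec.imdct_step3_inner_s_loop_ld654.Seg3 Lay μ u₀ :=
  L.h_imdct_step3_inner_s_loop_ld654_3 Lay hLay μ hμ u₀ hcode.imdct_step3_inner_s_loop_ld654

/-- **The contract of `imdct_step3_inner_s_loop_ld654`**, from the composition of its segments (`imdct_step3_inner_s_loop_ld654.COMPOSITION`). -/
theorem ctr_imdct_step3_inner_s_loop_ld654 (L : Final.Leaves) (Lay : Layout) (hLay : Lay.hi = 0x1000000) (μ : Microarch) (hμ : UserX.MicroOK μ) (u₀ : State)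
    (hcode : AllCode Lay u₀) :
    ∀ (others : List Obj) (frames : List (Nat × FrameLayout)) (len i0 : Nat), Calls Lay μ Vorbis.WayInv (Vorbis.conv u₀) Vorbis.L.imdct_step3_inner_s_loop_ld654.entry (Vorbis.Spec.imdct_step3_inner_s_loop_ld654.spec others frames len i0) :=
  Vorbis.Spec.Worked.imdct_step3_inner_s_loop_ld654_COMPOSITION_ok Lay hLay μ hμ u₀
    (seg_imdct_step3_inner_s_loop_ld654_1 L Lay hLay μ hμ u₀ hcode)
    (seg_imdct_step3_inner_s_loop_ld654_2 L Lay hLay μ hμ u₀ hcode)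
    (seg_imdct_step3_inner_s_loop_ld654_3 L Lay hLay μ hμ u₀ hcode)

/-- **The contract of `arena_unpoison`**, from the unit `arena_unpoison`. -/
theorem ctr_arena_unpoison (L : Final.Leaves) (Lay : Layout) (hLay : Lay.hi = 0x1000000) (μ : Microarch) (hμ : UserX.MicroOK μ) (u₀ : State)
    (hcode : AllCode Lay u₀) :
    Calls Lay μ Vorbis.WayInv (Vorbis.conv u₀) Vorbis.L.arena_unpoison.entry Asan.arenaUnpoisonSpec :=
  L.h_arena_unpoison Lay hLay μ hμ u₀ hcode.arena_unpoison

/-- **The contract of `malloc`**, from the unit `malloc`. -/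
theorem ctr_malloc (L : Final.Leaves) (Lay : Layout) (hLay : Lay.hi = 0x1000000) (μ : Microarch) (hμ : UserX.MicroOK μ) (u₀ : State)
    (hcode : AllCode Lay u₀) :
    ∀ (others : List Obj) (frames : List (Nat × FrameLayout)), Calls Lay μ Vorbis.WayInv (Vorbis.conv u₀) Vorbis.L.malloc.entry (Vorbis.Spec.malloc.spec others frames) :=
  L.h_malloc Lay hLay μ hμ u₀ hcode.malloc

/-- **The contract of `setup_temp_malloc`**, from the unit `setup_temp_malloc`. -/
theorem ctr_setup_temp_malloc (L : Final.Leaves) (Lay : Layout) (hLay : Lay.hi = 0x1000000) (μ : Microarch) (hμ : UserX.MicroOK μ) (u₀ : State)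
    (hcode : AllCode Lay u₀) :
    ∀ (others : List Obj) (frames : List (Nat × FrameLayout)) (A : Arena), Calls Lay μ Vorbis.WayInv (Vorbis.conv u₀) Vorbis.L.setup_temp_malloc.entry (Vorbis.Spec.setup_temp_malloc.spec others frames A) :=
  L.h_setup_temp_malloc Lay hLay μ hμ u₀ hcode.setup_temp_malloc
    (ctr_asan_load8_noabort L Lay hLay μ hμ u₀ hcode)
    (ctr_asan_load4_noabort L Lay hLay μ hμ u₀ hcode)
    (ctr_arena_unpoison L Lay hLay μ hμ u₀ hcode)
    (ctr_malloc L Lay hLay μ hμ u₀ hcode)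

/-- **The contract of `arena_poison`**, from the unit `arena_poison`. -/
theorem ctr_arena_poison (L : Final.Leaves) (Lay : Layout) (hLay : Lay.hi = 0x1000000) (μ : Microarch) (hμ : UserX.MicroOK μ) (u₀ : State)
    (hcode : AllCode Lay u₀) :
    Calls Lay μ Vorbis.WayInv (Vorbis.conv u₀) Vorbis.L.arena_poison.entry Asan.arenaPoisonSpec :=
  L.h_arena_poison Lay hLay μ hμ u₀ hcode.arena_poison

/-- **The contract of `arena_temp_restore`**, from the unit `arena_temp_restore`. -/
theorem ctr_arena_temp_restore (L : Final.Leaves) (Lay : Layout) (hLay : Lay.hi = 0x1000000) (μ : Microarch) (hμ : UserX.MicroOK μ) (u₀ : State)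
    (hcode : AllCode Lay u₀) :
    ∀ (others : List Obj) (frames : List (Nat × FrameLayout)) (A : Arena) (dead keep : List (Nat × Nat)), Calls Lay μ Vorbis.WayInv (Vorbis.conv u₀) Vorbis.L.arena_temp_restore.entry (Vorbis.Spec.arena_temp_restore.spec others frames A dead keep) :=
  L.h_arena_temp_restore Lay hLay μ hμ u₀ hcode.arena_temp_restore
    (ctr_asan_load8_noabort L Lay hLay μ hμ u₀ hcode)
    (ctr_asan_load4_noabort L Lay hLay μ hμ u₀ hcode)
    (ctr_arena_poison L Lay hLay μ hμ u₀ hcode)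
    (ctr_asan_store4_noabort L Lay hLay μ hμ u₀ hcode)

/-- Segment `inverse_mdct.1` of `inverse_mdct`: its claim, from the unit's statement. -/
theorem seg_inverse_mdct_1 (L : Final.Leaves) (Lay : Layout) (hLay : Lay.hi = 0x1000000) (μ : Microarch) (hμ : UserX.MicroOK μ) (u₀ : State)
    (hcode : AllCode Lay u₀) :
    Vorbis.Spec.inverse_mdct.Seg1 Lay μ u₀ :=
  L.h_inverse_mdct_1 Lay hLay μ hμ u₀ hcode.inverse_mdct
    (ctr_asan_load4_noabort L Lay hLay μ hμ u₀ hcode)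
    (ctr_asan_load8_noabort L Lay hLay μ hμ u₀ hcode)
    (ctr_setup_temp_malloc L Lay hLay μ hμ u₀ hcode)

/-- Segment `inverse_mdct.2` of `inverse_mdct`: its claim, from the unit's statement. -/
theorem seg_inverse_mdct_2 (L : Final.Leaves) (Lay : Layout) (hLay : Lay.hi = 0x1000000) (μ : Microarch) (hμ : UserX.MicroOK μ) (u₀ : State)
    (hcode : AllCode Lay u₀) :
    Vorbis.Spec.inverse_mdct.Seg2 Lay μ u₀ :=
  L.h_inverse_mdct_2 Lay hLay μ hμ u₀ hcode.inverse_mdct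
    (ctr_asan_load4_noabort L Lay hLay μ hμ u₀ hcode)
    (ctr_asan_store4_noabort L Lay hLay μ hμ u₀ hcode)

/-- Segment `inverse_mdct.3` of `inverse_mdct`: its claim, from the unit's statement. -/
theorem seg_inverse_mdct_3 (L : Final.Leaves) (Lay : Layout) (hLay : Lay.hi = 0x1000000) (μ : Microarch) (hμ : UserX.MicroOK μ) (u₀ : State)
    (hcode : AllCode Lay u₀) :
    Vorbis.Spec.inverse_mdct.Seg3 Lay μ u₀ :=
  L.h_inverse_mdct_3 Lay hLay μ hμ u₀ hcode.inverse_mdct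
    (ctr_asan_load4_noabort L Lay hLay μ hμ u₀ hcode)
    (ctr_asan_store4_noabort L Lay hLay μ hμ u₀ hcode)

/-- Segment `inverse_mdct.4` of `inverse_mdct`: its claim, from the unit's statement. -/
theorem seg_inverse_mdct_4 (L : Final.Leaves) (Lay : Layout) (hLay : Lay.hi = 0x1000000) (μ : Microarch) (hμ : UserX.MicroOK μ) (u₀ : State)
    (hcode : AllCode Lay u₀) :
    Vorbis.Spec.inverse_mdct.Seg4 Lay μ u₀ :=
  L.h_inverse_mdct_4 Lay hLay μ hμ u₀ hcode.inverse_mdct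
    (ctr_asan_load4_noabort L Lay hLay μ hμ u₀ hcode)
    (ctr_asan_store4_noabort L Lay hLay μ hμ u₀ hcode)

/-- Segment `inverse_mdct.5` of `inverse_mdct`: its claim, from the unit's statement. -/
theorem seg_inverse_mdct_5 (L : Final.Leaves) (Lay : Layout) (hLay : Lay.hi = 0x1000000) (μ : Microarch) (hμ : UserX.MicroOK μ) (u₀ : State)
    (hcode : AllCode Lay u₀) :
    Vorbis.Spec.inverse_mdct.Seg5 Lay μ u₀ :=
  L.h_inverse_mdct_5 Lay hLay μ hμ u₀ hcode.inverse_mdct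
    (ctr_ilog L Lay hLay μ hμ u₀ hcode)
    (ctr_imdct_step3_iter0_loop L Lay hLay μ hμ u₀ hcode)
    (ctr_imdct_step3_inner_r_loop L Lay hLay μ hμ u₀ hcode)

/-- Segment `inverse_mdct.6` of `inverse_mdct`: its claim, from the unit's statement. -/
theorem seg_inverse_mdct_6 (L : Final.Leaves) (Lay : Layout) (hLay : Lay.hi = 0x1000000) (μ : Microarch) (hμ : UserX.MicroOK μ) (u₀ : State)
    (hcode : AllCode Lay u₀) :
    Vorbis.Spec.inverse_mdct.Seg6 Lay μ u₀ :=
  L.h_inverse_mdct_6 Lay hLay μ hμ u₀ hcode.inverse_mdct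
    (ctr_imdct_step3_inner_r_loop L Lay hLay μ hμ u₀ hcode)

/-- Segment `inverse_mdct.7` of `inverse_mdct`: its claim, from the unit's statement. -/
theorem seg_inverse_mdct_7 (L : Final.Leaves) (Lay : Layout) (hLay : Lay.hi = 0x1000000) (μ : Microarch) (hμ : UserX.MicroOK μ) (u₀ : State)
    (hcode : AllCode Lay u₀) :
    Vorbis.Spec.inverse_mdct.Seg7 Lay μ u₀ :=
  (stmt_inverse_mdct_7 L) Lay hLay μ hμ u₀ hcode.inverse_mdct
    (ctr_imdct_step3_inner_s_loop L Lay hLay μ hμ u₀ hcode)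
    (ctr_imdct_step3_inner_s_loop_ld654 L Lay hLay μ hμ u₀ hcode)
    (ctr_asan_load8_noabort L Lay hLay μ hμ u₀ hcode)

/-- Segment `inverse_mdct.8` of `inverse_mdct`: its claim, from the unit's statement. -/
theorem seg_inverse_mdct_8 (L : Final.Leaves) (Lay : Layout) (hLay : Lay.hi = 0x1000000) (μ : Microarch) (hμ : UserX.MicroOK μ) (u₀ : State)
    (hcode : AllCode Lay u₀) :
    Vorbis.Spec.inverse_mdct.Seg8 Lay μ u₀ :=
  L.h_inverse_mdct_8 Lay hLay μ hμ u₀ hcode.inverse_mdct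
    (ctr_asan_load2_noabort L Lay hLay μ hμ u₀ hcode)
    (ctr_asan_load4_noabort L Lay hLay μ hμ u₀ hcode)
    (ctr_asan_store4_noabort L Lay hLay μ hμ u₀ hcode)
    (ctr_asan_load8_noabort L Lay hLay μ hμ u₀ hcode)

/-- Segment `inverse_mdct.9` of `inverse_mdct`: its claim, from the unit's statement. -/
theorem seg_inverse_mdct_9 (L : Final.Leaves) (Lay : Layout) (hLay : Lay.hi = 0x1000000) (μ : Microarch) (hμ : UserX.MicroOK μ) (u₀ : State)
    (hcode : AllCode Lay u₀) :
    Vorbis.Spec.inverse_mdct.Seg9 Lay μ u₀ :=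
  L.h_inverse_mdct_9 Lay hLay μ hμ u₀ hcode.inverse_mdct
    (ctr_asan_load4_noabort L Lay hLay μ hμ u₀ hcode)
    (ctr_asan_load8_noabort L Lay hLay μ hμ u₀ hcode)

/-- Segment `inverse_mdct.10` of `inverse_mdct`: its claim, from the unit's statement. -/
theorem seg_inverse_mdct_10 (L : Final.Leaves) (Lay : Layout) (hLay : Lay.hi = 0x1000000) (μ : Microarch) (hμ : UserX.MicroOK μ) (u₀ : State)
    (hcode : AllCode Lay u₀) :
    Vorbis.Spec.inverse_mdct.Seg10 Lay μ u₀ :=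
  L.h_inverse_mdct_10 Lay hLay μ hμ u₀ hcode.inverse_mdct
    (ctr_asan_load4_noabort L Lay hLay μ hμ u₀ hcode)
    (ctr_asan_store4_noabort L Lay hLay μ hμ u₀ hcode)

/-- Segment `inverse_mdct.11` of `inverse_mdct`: its claim, from the unit's statement. -/
theorem seg_inverse_mdct_11 (L : Final.Leaves) (Lay : Layout) (hLay : Lay.hi = 0x1000000) (μ : Microarch) (hμ : UserX.MicroOK μ) (u₀ : State)
    (hcode : AllCode Lay u₀) :
    Vorbis.Spec.inverse_mdct.Seg11 Lay μ u₀ :=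
  L.h_inverse_mdct_11 Lay hLay μ hμ u₀ hcode.inverse_mdct
    (ctr_asan_load4_noabort L Lay hLay μ hμ u₀ hcode)
    (ctr_asan_store4_noabort L Lay hLay μ hμ u₀ hcode)

/-- Segment `inverse_mdct.12` of `inverse_mdct`: its claim, from the unit's statement. -/
theorem seg_inverse_mdct_12 (L : Final.Leaves) (Lay : Layout) (hLay : Lay.hi = 0x1000000) (μ : Microarch) (hμ : UserX.MicroOK μ) (u₀ : State)
    (hcode : AllCode Lay u₀) :
    Vorbis.Spec.inverse_mdct.Seg12 Lay μ u₀ :=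
  L.h_inverse_mdct_12 Lay hLay μ hμ u₀ hcode.inverse_mdct
    (ctr_arena_temp_restore L Lay hLay μ hμ u₀ hcode)

/-- **The contract of `inverse_mdct`**, from the composition of its segments (`inverse_mdct.COMPOSITION`). -/
theorem ctr_inverse_mdct (L : Final.Leaves) (Lay : Layout) (hLay : Lay.hi = 0x1000000) (μ : Microarch) (hμ : UserX.MicroOK μ) (u₀ : State)
    (hcode : AllCode Lay u₀) :
    ∀ (others : List Obj) (frames : List (Nat × FrameLayout)) (len : Nat) (A : Arena) (stored room : Int) (ysz : Nat → Nat) (k c : Nat), Calls Lay μ Vorbis.WayInv (Vorbis.conv u₀) Vorbis.L.inverse_mdct.entry (Vorbis.Spec.inverse_mdct.spec others frames len A stored room ysz k c) :=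
  Vorbis.Spec.Worked.inverse_mdct_COMPOSITION_ok Lay hLay μ hμ u₀
    (seg_inverse_mdct_1 L Lay hLay μ hμ u₀ hcode)
    (seg_inverse_mdct_2 L Lay hLay μ hμ u₀ hcode)
    (seg_inverse_mdct_3 L Lay hLay μ hμ u₀ hcode)
    (seg_inverse_mdct_4 L Lay hLay μ hμ u₀ hcode)
    (seg_inverse_mdct_5 L Lay hLay μ hμ u₀ hcode)
    (seg_inverse_mdct_6 L Lay hLay μ hμ u₀ hcode)
    (seg_inverse_mdct_7 L Lay hLay μ hμ u₀ hcode)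
    (seg_inverse_mdct_8 L Lay hLay μ hμ u₀ hcode)
    (seg_inverse_mdct_9 L Lay hLay μ hμ u₀ hcode)
    (seg_inverse_mdct_10 L Lay hLay μ hμ u₀ hcode)
    (seg_inverse_mdct_11 L Lay hLay μ hμ u₀ hcode)
    (seg_inverse_mdct_12 L Lay hLay μ hμ u₀ hcode)

/-- **The contract of `get8`**, from the unit `get8`. -/
theorem ctr_get8 (L : Final.Leaves) (Lay : Layout) (hLay : Lay.hi = 0x1000000) (μ : Microarch) (hμ : UserX.MicroOK μ) (u₀ : State)
    (hcode : AllCode Lay u₀) :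
    ∀ (others : List Obj) (frames : List (Nat × FrameLayout)) (Blk : Block → Prop) (len : Nat), Calls Lay μ Vorbis.WayInv (Vorbis.conv u₀) Vorbis.L.get8.entry (Vorbis.Spec.get8.spec others frames Blk len) :=
  L.h_get8 Lay hLay μ hμ u₀ hcode.get8
    (ctr_asan_load8_noabort L Lay hLay μ hμ u₀ hcode)
    (ctr_asan_store4_noabort L Lay hLay μ hμ u₀ hcode)
    (ctr_asan_load1_noabort L Lay hLay μ hμ u₀ hcode)

/-- **The contract of `capture_pattern`**, from the unit `capture_pattern`. -/
theorem ctr_capture_pattern (L : Final.Leaves) (Lay : Layout) (hLay : Lay.hi = 0x1000000) (μ : Microarch) (hμ : UserX.MicroOK μ) (u₀ : State)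
    (hcode : AllCode Lay u₀) :
    ∀ (others : List Obj) (frames : List (Nat × FrameLayout)) (Blk : Block → Prop) (len : Nat), Calls Lay μ Vorbis.WayInv (Vorbis.conv u₀) Vorbis.L.capture_pattern.entry (Vorbis.Spec.capture_pattern.spec others frames Blk len) :=
  L.h_capture_pattern Lay hLay μ hμ u₀ hcode.capture_pattern
    (ctr_get8 L Lay hLay μ hμ u₀ hcode)

/-- **The contract of `get32`**, from the unit `get32`. -/
theorem ctr_get32 (L : Final.Leaves) (Lay : Layout) (hLay : Lay.hi = 0x1000000) (μ : Microarch) (hμ : UserX.MicroOK μ) (u₀ : State)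
    (hcode : AllCode Lay u₀) :
    ∀ (others : List Obj) (frames : List (Nat × FrameLayout)) (Blk : Block → Prop) (len : Nat), Calls Lay μ Vorbis.WayInv (Vorbis.conv u₀) Vorbis.L.get32.entry (Vorbis.Spec.get32.spec others frames Blk len) :=
  L.h_get32 Lay hLay μ hμ u₀ hcode.get32
    (ctr_get8 L Lay hLay μ hμ u₀ hcode)

/-- **The contract of `getn`**, from the unit `getn`. -/
theorem ctr_getn (L : Final.Leaves) (Lay : Layout) (hLay : Lay.hi = 0x1000000) (μ : Microarch) (hμ : UserX.MicroOK μ) (u₀ : State)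
    (hcode : AllCode Lay u₀) :
    ∀ (others : List Obj) (frames : List (Nat × FrameLayout)) (Blk : Block → Prop) (len : Nat), Calls Lay μ Vorbis.WayInv (Vorbis.conv u₀) Vorbis.L.getn.entry (Vorbis.Spec.getn.spec others frames Blk len) :=
  L.h_getn Lay hLay μ hμ u₀ hcode.getn
    (ctr_asan_load8_noabort L Lay hLay μ hμ u₀ hcode)
    (ctr_asan_store4_noabort L Lay hLay μ hμ u₀ hcode)
    (ctr_memcpy L Lay hLay μ hμ u₀ hcode)

/-- **The contract of `stb_vorbis_get_file_offset`**, from the unit `stb_vorbis_get_file_offset`. -/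
theorem ctr_stb_vorbis_get_file_offset (L : Final.Leaves) (Lay : Layout) (hLay : Lay.hi = 0x1000000) (μ : Microarch) (hμ : UserX.MicroOK μ) (u₀ : State)
    (hcode : AllCode Lay u₀) :
    ∀ (others : List Obj) (frames : List (Nat × FrameLayout)), Calls Lay μ Vorbis.WayInv (Vorbis.conv u₀) Vorbis.L.stb_vorbis_get_file_offset.entry (Vorbis.Spec.stb_vorbis_get_file_offset.spec others frames) :=
  L.h_stb_vorbis_get_file_offset Lay hLay μ hμ u₀ hcode.stb_vorbis_get_file_offset
    (ctr_asan_load8_noabort L Lay hLay μ hμ u₀ hcode)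

/-- **The contract of `start_page_no_capturepattern`**, from the unit `start_page_no_capturepattern`. -/
theorem ctr_start_page_no_capturepattern (L : Final.Leaves) (Lay : Layout) (hLay : Lay.hi = 0x1000000) (μ : Microarch) (hμ : UserX.MicroOK μ) (u₀ : State)
    (hcode : AllCode Lay u₀) :
    ∀ (others : List Obj) (frames : List (Nat × FrameLayout)) (Blk : Block → Prop) (len : Nat), Calls Lay μ Vorbis.WayInv (Vorbis.conv u₀) Vorbis.L.start_page_no_capturepattern.entry (Vorbis.Spec.start_page_no_capturepattern.spec others frames Blk len) :=
  L.h_start_page_no_capturepattern Lay hLay μ hμ u₀ hcode.start_page_no_capturepattern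
    (ctr_asan_load1_noabort L Lay hLay μ hμ u₀ hcode)
    (ctr_stb_vorbis_get_file_offset L Lay hLay μ hμ u₀ hcode)
    (ctr_asan_store4_noabort L Lay hLay μ hμ u₀ hcode)
    (ctr_get8 L Lay hLay μ hμ u₀ hcode)
    (ctr_asan_store1_noabort L Lay hLay μ hμ u₀ hcode)
    (ctr_get32 L Lay hLay μ hμ u₀ hcode)
    (ctr_getn L Lay hLay μ hμ u₀ hcode)
    (ctr_asan_load4_noabort L Lay hLay μ hμ u₀ hcode)
    (ctr_error L Lay hLay μ hμ u₀ hcode)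

/-- **The contract of `start_page`**, from the unit `start_page`. -/
theorem ctr_start_page (L : Final.Leaves) (Lay : Layout) (hLay : Lay.hi = 0x1000000) (μ : Microarch) (hμ : UserX.MicroOK μ) (u₀ : State)
    (hcode : AllCode Lay u₀) :
    ∀ (others : List Obj) (frames : List (Nat × FrameLayout)) (Blk : Block → Prop) (len : Nat), Calls Lay μ Vorbis.WayInv (Vorbis.conv u₀) Vorbis.L.start_page.entry (Vorbis.Spec.start_page.spec others frames Blk len) :=
  L.h_start_page Lay hLay μ hμ u₀ hcode.start_page
    (ctr_capture_pattern L Lay hLay μ hμ u₀ hcode)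
    (ctr_start_page_no_capturepattern L Lay hLay μ hμ u₀ hcode)
    (ctr_error L Lay hLay μ hμ u₀ hcode)

/-- **The contract of `next_segment`**, from the unit `next_segment`. -/
theorem ctr_next_segment (L : Final.Leaves) (Lay : Layout) (hLay : Lay.hi = 0x1000000) (μ : Microarch) (hμ : UserX.MicroOK μ) (u₀ : State)
    (hcode : AllCode Lay u₀) :
    ∀ (others : List Obj) (frames : List (Nat × FrameLayout)) (Blk : Block → Prop) (len : Nat), Calls Lay μ Vorbis.WayInv (Vorbis.conv u₀) Vorbis.L.next_segment.entry (Vorbis.Spec.next_segment.spec others frames Blk len) :=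
  L.h_next_segment Lay hLay μ hμ u₀ hcode.next_segment
    (ctr_asan_load4_noabort L Lay hLay μ hμ u₀ hcode)
    (ctr_asan_load1_noabort L Lay hLay μ hμ u₀ hcode)
    (ctr_asan_store4_noabort L Lay hLay μ hμ u₀ hcode)
    (ctr_asan_store1_noabort L Lay hLay μ hμ u₀ hcode)
    (ctr_start_page L Lay hLay μ hμ u₀ hcode)
    (ctr_error L Lay hLay μ hμ u₀ hcode)

/-- **The contract of `get8_packet_raw`**, from the unit `get8_packet_raw`. -/
theorem ctr_get8_packet_raw (L : Final.Leaves) (Lay : Layout) (hLay : Lay.hi = 0x1000000) (μ : Microarch) (hμ : UserX.MicroOK μ) (u₀ : State)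
    (hcode : AllCode Lay u₀) :
    ∀ (others : List Obj) (frames : List (Nat × FrameLayout)) (Blk : Block → Prop) (len : Nat), Calls Lay μ Vorbis.WayInv (Vorbis.conv u₀) Vorbis.L.get8_packet_raw.entry (Vorbis.Spec.get8_packet_raw.spec others frames Blk len) :=
  L.h_get8_packet_raw Lay hLay μ hμ u₀ hcode.get8_packet_raw
    (ctr_asan_load1_noabort L Lay hLay μ hμ u₀ hcode)
    (ctr_asan_load4_noabort L Lay hLay μ hμ u₀ hcode)
    (ctr_next_segment L Lay hLay μ hμ u₀ hcode)
    (ctr_get8 L Lay hLay μ hμ u₀ hcode)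

/-- The contract `get_bits.spec24`, from the unit `get_bits.24`. -/
theorem ctr_get_bits_24 (L : Final.Leaves) (Lay : Layout) (hLay : Lay.hi = 0x1000000) (μ : Microarch) (hμ : UserX.MicroOK μ) (u₀ : State)
    (hcode : AllCode Lay u₀) :
    ∀ (others : List Obj) (frames : List (Nat × FrameLayout)) (Blk : Block → Prop) (len : Nat), Calls Lay μ Vorbis.WayInv (Vorbis.conv u₀) Vorbis.L.get_bits.entry (Vorbis.Spec.get_bits.spec24 others frames Blk len) :=
  L.h_get_bits_24 Lay hLay μ hμ u₀ hcode.get_bits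
    (ctr_asan_load4_noabort L Lay hLay μ hμ u₀ hcode)
    (ctr_asan_store4_noabort L Lay hLay μ hμ u₀ hcode)
    (ctr_get8_packet_raw L Lay hLay μ hμ u₀ hcode)

/-- **The contract of `get_bits`**, from the unit `get_bits`. -/
theorem ctr_get_bits (L : Final.Leaves) (Lay : Layout) (hLay : Lay.hi = 0x1000000) (μ : Microarch) (hμ : UserX.MicroOK μ) (u₀ : State)
    (hcode : AllCode Lay u₀) :
    ∀ (others : List Obj) (frames : List (Nat × FrameLayout)) (Blk : Block → Prop) (len : Nat), Calls Lay μ Vorbis.WayInv (Vorbis.conv u₀) Vorbis.L.get_bits.entry (Vorbis.Spec.get_bits.spec others frames Blk len) :=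
  L.h_get_bits Lay hLay μ hμ u₀ hcode.get_bits
    (ctr_asan_load4_noabort L Lay hLay μ hμ u₀ hcode)
    (ctr_asan_store4_noabort L Lay hLay μ hμ u₀ hcode)
    (ctr_get8_packet_raw L Lay hLay μ hμ u₀ hcode)
    (ctr_get_bits_24 L Lay hLay μ hμ u₀ hcode)

/-- **The contract of `prep_huffman`**, from the unit `prep_huffman`. -/
theorem ctr_prep_huffman (L : Final.Leaves) (Lay : Layout) (hLay : Lay.hi = 0x1000000) (μ : Microarch) (hμ : UserX.MicroOK μ) (u₀ : State)
    (hcode : AllCode Lay u₀) :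
    ∀ (others : List Obj) (frames : List (Nat × FrameLayout)) (Blk : Block → Prop) (len : Nat), Calls Lay μ Vorbis.WayInv (Vorbis.conv u₀) Vorbis.L.prep_huffman.entry (Vorbis.Spec.prep_huffman.spec others frames Blk len) :=
  L.h_prep_huffman Lay hLay μ hμ u₀ hcode.prep_huffman
    (ctr_asan_load4_noabort L Lay hLay μ hμ u₀ hcode)
    (ctr_asan_store4_noabort L Lay hLay μ hμ u₀ hcode)
    (ctr_get8_packet_raw L Lay hLay μ hμ u₀ hcode)
    (ctr_asan_load1_noabort L Lay hLay μ hμ u₀ hcode)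

/-- **The contract of `bit_reverse`**, from the unit `bit_reverse`. -/
theorem ctr_bit_reverse (L : Final.Leaves) (Lay : Layout) (hLay : Lay.hi = 0x1000000) (μ : Microarch) (hμ : UserX.MicroOK μ) (u₀ : State)
    (hcode : AllCode Lay u₀) :
    ∀ (others : List Obj) (frames : List (Nat × FrameLayout)), Calls Lay μ Vorbis.WayInv (Vorbis.conv u₀) Vorbis.L.bit_reverse.entry (Vorbis.Spec.bit_reverse.spec others frames) :=
  L.h_bit_reverse Lay hLay μ hμ u₀ hcode.bit_reverse

/-- Segment `codebook_decode_scalar_raw.1` of `codebook_decode_scalar_raw`: its claim, from the unit's statement. -/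
theorem seg_codebook_decode_scalar_raw_1 (L : Final.Leaves) (Lay : Layout) (hLay : Lay.hi = 0x1000000) (μ : Microarch) (hμ : UserX.MicroOK μ) (u₀ : State)
    (hcode : AllCode Lay u₀) :
    Vorbis.Spec.ScalarRaw.Claim1 Lay μ u₀ :=
  L.h_codebook_decode_scalar_raw_1 Lay hLay μ hμ u₀ hcode.codebook_decode_scalar_raw
    (ctr_prep_huffman L Lay hLay μ hμ u₀ hcode)
    (ctr_asan_load8_noabort L Lay hLay μ hμ u₀ hcode)
    (ctr_asan_load4_noabort L Lay hLay μ hμ u₀ hcode)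

/-- Segment `codebook_decode_scalar_raw.2` of `codebook_decode_scalar_raw`: its claim, from the unit's statement. -/
theorem seg_codebook_decode_scalar_raw_2 (L : Final.Leaves) (Lay : Layout) (hLay : Lay.hi = 0x1000000) (μ : Microarch) (hμ : UserX.MicroOK μ) (u₀ : State)
    (hcode : AllCode Lay u₀) :
    Vorbis.Spec.ScalarRaw.Claim2 Lay μ u₀ :=
  L.h_codebook_decode_scalar_raw_2 Lay hLay μ hμ u₀ hcode.codebook_decode_scalar_raw
    (ctr_asan_load4_noabort L Lay hLay μ hμ u₀ hcode)
    (ctr_bit_reverse L Lay hLay μ hμ u₀ hcode)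
    (ctr_asan_load8_noabort L Lay hLay μ hμ u₀ hcode)
    (ctr_asan_load1_noabort L Lay hLay μ hμ u₀ hcode)
    (ctr_asan_store4_noabort L Lay hLay μ hμ u₀ hcode)

/-- Segment `codebook_decode_scalar_raw.3` of `codebook_decode_scalar_raw`: its claim, from the unit's statement. -/
theorem seg_codebook_decode_scalar_raw_3 (L : Final.Leaves) (Lay : Layout) (hLay : Lay.hi = 0x1000000) (μ : Microarch) (hμ : UserX.MicroOK μ) (u₀ : State)
    (hcode : AllCode Lay u₀) :
    Vorbis.Spec.ScalarRaw.Claim3 Lay μ u₀ :=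
  L.h_codebook_decode_scalar_raw_3 Lay hLay μ hμ u₀ hcode.codebook_decode_scalar_raw
    (ctr_asan_load8_noabort L Lay hLay μ hμ u₀ hcode)
    (ctr_asan_load1_noabort L Lay hLay μ hμ u₀ hcode)
    (ctr_asan_load4_noabort L Lay hLay μ hμ u₀ hcode)
    (ctr_error L Lay hLay μ hμ u₀ hcode)
    (ctr_asan_store4_noabort L Lay hLay μ hμ u₀ hcode)

/-- Segment `codebook_decode_scalar_raw.4` of `codebook_decode_scalar_raw`: its claim, from the unit's statement. -/
theorem seg_codebook_decode_scalar_raw_4 (L : Final.Leaves) (Lay : Layout) (hLay : Lay.hi = 0x1000000) (μ : Microarch) (hμ : UserX.MicroOK μ) (u₀ : State)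
    (hcode : AllCode Lay u₀) :
    Vorbis.Spec.ScalarRaw.Claim4 Lay μ u₀ :=
  L.h_codebook_decode_scalar_raw_4 Lay hLay μ hμ u₀ hcode.codebook_decode_scalar_raw

/-- **The contract of `codebook_decode_scalar_raw`**, from the composition of its segments (`codebook_decode_scalar_raw.COMPOSITION`). -/
theorem ctr_codebook_decode_scalar_raw (L : Final.Leaves) (Lay : Layout) (hLay : Lay.hi = 0x1000000) (μ : Microarch) (hμ : UserX.MicroOK μ) (u₀ : State)
    (hcode : AllCode Lay u₀) :
    ∀ (others : List Obj) (frames : List (Nat × FrameLayout)) (Blk : Block → Prop) (len : Nat), Calls Lay μ Vorbis.WayInv (Vorbis.conv u₀) Vorbis.L.codebook_decode_scalar_raw.entry (Vorbis.Spec.codebook_decode_scalar_raw.spec others frames Blk len) :=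
  Vorbis.Spec.Worked.codebook_decode_scalar_raw_COMPOSITION_ok Lay hLay μ hμ u₀
    (seg_codebook_decode_scalar_raw_1 L Lay hLay μ hμ u₀ hcode)
    (seg_codebook_decode_scalar_raw_2 L Lay hLay μ hμ u₀ hcode)
    (seg_codebook_decode_scalar_raw_3 L Lay hLay μ hμ u₀ hcode)
    (seg_codebook_decode_scalar_raw_4 L Lay hLay μ hμ u₀ hcode)

/-- **The contract of `make_block_array`**, from the unit `make_block_array`. -/
theorem ctr_make_block_array (L : Final.Leaves) (Lay : Layout) (hLay : Lay.hi = 0x1000000) (μ : Microarch) (hμ : UserX.MicroOK μ) (u₀ : State)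
    (hcode : AllCode Lay u₀) :
    ∀ (others : List Obj) (frames : List (Nat × FrameLayout)), Calls Lay μ Vorbis.WayInv (Vorbis.conv u₀) Vorbis.L.make_block_array.entry (Vorbis.Spec.make_block_array.spec others frames) :=
  L.h_make_block_array Lay hLay μ hμ u₀ hcode.make_block_array
    (ctr_asan_store8_noabort L Lay hLay μ hμ u₀ hcode)

/-- Segment `codebook_decode_deinterleave_repeat.1` of `codebook_decode_deinterleave_repeat`: its claim, from the unit's statement. -/
theorem seg_codebook_decode_deinterleave_repeat_1 (L : Final.Leaves) (Lay : Layout) (hLay : Lay.hi = 0x1000000) (μ : Microarch) (hμ : UserX.MicroOK μ) (u₀ : State)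
    (hcode : AllCode Lay u₀) :
    Vorbis.Spec.Deint.Claim1 Lay μ u₀ :=
  L.h_codebook_decode_deinterleave_repeat_1 Lay hLay μ hμ u₀ hcode.codebook_decode_deinterleave_repeat
    (ctr_asan_load4_noabort L Lay hLay μ hμ u₀ hcode)
    (ctr_asan_load1_noabort L Lay hLay μ hμ u₀ hcode)
    (ctr_error L Lay hLay μ hμ u₀ hcode)

/-- Segment `codebook_decode_deinterleave_repeat.2` of `codebook_decode_deinterleave_repeat`: its claim, from the unit's statement. -/
theorem seg_codebook_decode_deinterleave_repeat_2 (L : Final.Leaves) (Lay : Layout) (hLay : Lay.hi = 0x1000000) (μ : Microarch) (hμ : UserX.MicroOK μ) (u₀ : State)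
    (hcode : AllCode Lay u₀) :
    Vorbis.Spec.Deint.Claim2 Lay μ u₀ :=
  (stmt_codebook_decode_deinterleave_repeat_2 L) Lay hLay μ hμ u₀ hcode.codebook_decode_deinterleave_repeat
    (ctr_prep_huffman L Lay hLay μ hμ u₀ hcode)
    (ctr_asan_load1_noabort L Lay hLay μ hμ u₀ hcode)
    (ctr_asan_load4_noabort L Lay hLay μ hμ u₀ hcode)
    (ctr_error L Lay hLay μ hμ u₀ hcode)
    (ctr_codebook_decode_scalar_raw L Lay hLay μ hμ u₀ hcode)
    (ctr_asan_load2_noabort L Lay hLay μ hμ u₀ hcode)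
    (ctr_asan_load8_noabort L Lay hLay μ hμ u₀ hcode)

/-- Segment `codebook_decode_deinterleave_repeat.3` of `codebook_decode_deinterleave_repeat`: its claim, from the unit's statement. -/
theorem seg_codebook_decode_deinterleave_repeat_3 (L : Final.Leaves) (Lay : Layout) (hLay : Lay.hi = 0x1000000) (μ : Microarch) (hμ : UserX.MicroOK μ) (u₀ : State)
    (hcode : AllCode Lay u₀) :
    Vorbis.Spec.Deint.Claim3 Lay μ u₀ :=
  L.h_codebook_decode_deinterleave_repeat_3 Lay hLay μ hμ u₀ hcode.codebook_decode_deinterleave_repeat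
    (ctr_asan_load8_noabort L Lay hLay μ hμ u₀ hcode)
    (ctr_asan_load4_noabort L Lay hLay μ hμ u₀ hcode)

/-- Segment `codebook_decode_deinterleave_repeat.4` of `codebook_decode_deinterleave_repeat`: its claim, from the unit's statement. -/
theorem seg_codebook_decode_deinterleave_repeat_4 (L : Final.Leaves) (Lay : Layout) (hLay : Lay.hi = 0x1000000) (μ : Microarch) (hμ : UserX.MicroOK μ) (u₀ : State)
    (hcode : AllCode Lay u₀) :
    Vorbis.Spec.Deint.Claim4 Lay μ u₀ :=
  L.h_codebook_decode_deinterleave_repeat_4 Lay hLay μ hμ u₀ hcode.codebook_decode_deinterleave_repeat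
    (ctr_asan_load8_noabort L Lay hLay μ hμ u₀ hcode)
    (ctr_asan_load4_noabort L Lay hLay μ hμ u₀ hcode)

/-- Segment `codebook_decode_deinterleave_repeat.5` of `codebook_decode_deinterleave_repeat`: its claim, from the unit's statement. -/
theorem seg_codebook_decode_deinterleave_repeat_5 (L : Final.Leaves) (Lay : Layout) (hLay : Lay.hi = 0x1000000) (μ : Microarch) (hμ : UserX.MicroOK μ) (u₀ : State)
    (hcode : AllCode Lay u₀) :
    Vorbis.Spec.Deint.Claim5 Lay μ u₀ :=
  L.h_codebook_decode_deinterleave_repeat_5 Lay hLay μ hμ u₀ hcode.codebook_decode_deinterleave_repeat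

/-- Segment `codebook_decode_deinterleave_repeat.6` of `codebook_decode_deinterleave_repeat`: its claim, from the unit's statement. -/
theorem seg_codebook_decode_deinterleave_repeat_6 (L : Final.Leaves) (Lay : Layout) (hLay : Lay.hi = 0x1000000) (μ : Microarch) (hμ : UserX.MicroOK μ) (u₀ : State)
    (hcode : AllCode Lay u₀) :
    Vorbis.Spec.Deint.Claim6 Lay μ u₀ :=
  L.h_codebook_decode_deinterleave_repeat_6 Lay hLay μ hμ u₀ hcode.codebook_decode_deinterleave_repeat
    (ctr_asan_store4_noabort L Lay hLay μ hμ u₀ hcode)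

/-- Segment `codebook_decode_deinterleave_repeat.7` of `codebook_decode_deinterleave_repeat`: its claim, from the unit's statement. -/
theorem seg_codebook_decode_deinterleave_repeat_7 (L : Final.Leaves) (Lay : Layout) (hLay : Lay.hi = 0x1000000) (μ : Microarch) (hμ : UserX.MicroOK μ) (u₀ : State)
    (hcode : AllCode Lay u₀) :
    Vorbis.Spec.Deint.Claim7 Lay μ u₀ :=
  L.h_codebook_decode_deinterleave_repeat_7 Lay hLay μ hμ u₀ hcode.codebook_decode_deinterleave_repeat

/-- **The contract of `codebook_decode_deinterleave_repeat`**, from the composition of its segments (`codebook_decode_deinterleave_repeat.COMPOSITION`). -/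
theorem ctr_codebook_decode_deinterleave_repeat (L : Final.Leaves) (Lay : Layout) (hLay : Lay.hi = 0x1000000) (μ : Microarch) (hμ : UserX.MicroOK μ) (u₀ : State)
    (hcode : AllCode Lay u₀) :
    ∀ (others : List Obj) (frames : List (Nat × FrameLayout)) (Blk : Block → Prop) (len : Nat), Calls Lay μ Vorbis.WayInv (Vorbis.conv u₀) Vorbis.L.codebook_decode_deinterleave_repeat.entry (Vorbis.Spec.codebook_decode_deinterleave_repeat.spec others frames Blk len) :=
  Vorbis.Spec.Worked.codebook_decode_deinterleave_repeat_COMPOSITION_ok Lay hLay μ hμ u₀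
    (seg_codebook_decode_deinterleave_repeat_1 L Lay hLay μ hμ u₀ hcode)
    (seg_codebook_decode_deinterleave_repeat_2 L Lay hLay μ hμ u₀ hcode)
    (seg_codebook_decode_deinterleave_repeat_3 L Lay hLay μ hμ u₀ hcode)
    (seg_codebook_decode_deinterleave_repeat_4 L Lay hLay μ hμ u₀ hcode)
    (seg_codebook_decode_deinterleave_repeat_5 L Lay hLay μ hμ u₀ hcode)
    (seg_codebook_decode_deinterleave_repeat_6 L Lay hLay μ hμ u₀ hcode)
    (seg_codebook_decode_deinterleave_repeat_7 L Lay hLay μ hμ u₀ hcode)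

/-- **The contract of `codebook_decode_start`**, from the unit `codebook_decode_start`. -/
theorem ctr_codebook_decode_start (L : Final.Leaves) (Lay : Layout) (hLay : Lay.hi = 0x1000000) (μ : Microarch) (hμ : UserX.MicroOK μ) (u₀ : State)
    (hcode : AllCode Lay u₀) :
    ∀ (others : List Obj) (frames : List (Nat × FrameLayout)) (Blk : Block → Prop) (len : Nat), Calls Lay μ Vorbis.WayInv (Vorbis.conv u₀) Vorbis.L.codebook_decode_start.entry (Vorbis.Spec.codebook_decode_start.spec others frames Blk len) :=
  L.h_codebook_decode_start Lay hLay μ hμ u₀ hcode.codebook_decode_start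
    (ctr_asan_load1_noabort L Lay hLay μ hμ u₀ hcode)
    (ctr_asan_load4_noabort L Lay hLay μ hμ u₀ hcode)
    (ctr_asan_load2_noabort L Lay hLay μ hμ u₀ hcode)
    (ctr_asan_load8_noabort L Lay hLay μ hμ u₀ hcode)
    (ctr_error L Lay hLay μ hμ u₀ hcode)
    (ctr_prep_huffman L Lay hLay μ hμ u₀ hcode)
    (ctr_codebook_decode_scalar_raw L Lay hLay μ hμ u₀ hcode)

/-- **The contract of `codebook_decode_step`**, from the unit `codebook_decode_step`. -/
theorem ctr_codebook_decode_step (L : Final.Leaves) (Lay : Layout) (hLay : Lay.hi = 0x1000000) (μ : Microarch) (hμ : UserX.MicroOK μ) (u₀ : State)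
    (hcode : AllCode Lay u₀) :
    ∀ (others : List Obj) (frames : List (Nat × FrameLayout)) (Blk : Block → Prop) (len : Nat), Calls Lay μ Vorbis.WayInv (Vorbis.conv u₀) Vorbis.L.codebook_decode_step.entry (Vorbis.Spec.codebook_decode_step.spec others frames Blk len) :=
  L.h_codebook_decode_step Lay hLay μ hμ u₀ hcode.codebook_decode_step
    (ctr_codebook_decode_start L Lay hLay μ hμ u₀ hcode)
    (ctr_asan_load4_noabort L Lay hLay μ hμ u₀ hcode)
    (ctr_asan_load8_noabort L Lay hLay μ hμ u₀ hcode)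
    (ctr_asan_load1_noabort L Lay hLay μ hμ u₀ hcode)

/-- **The contract of `codebook_decode`**, from the unit `codebook_decode`. -/
theorem ctr_codebook_decode (L : Final.Leaves) (Lay : Layout) (hLay : Lay.hi = 0x1000000) (μ : Microarch) (hμ : UserX.MicroOK μ) (u₀ : State)
    (hcode : AllCode Lay u₀) :
    ∀ (others : List Obj) (frames : List (Nat × FrameLayout)) (Blk : Block → Prop) (len : Nat), Calls Lay μ Vorbis.WayInv (Vorbis.conv u₀) Vorbis.L.codebook_decode.entry (Vorbis.Spec.codebook_decode.spec others frames Blk len) :=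
  L.h_codebook_decode Lay hLay μ hμ u₀ hcode.codebook_decode
    (ctr_codebook_decode_start L Lay hLay μ hμ u₀ hcode)
    (ctr_asan_load4_noabort L Lay hLay μ hμ u₀ hcode)
    (ctr_asan_load1_noabort L Lay hLay μ hμ u₀ hcode)
    (ctr_asan_load8_noabort L Lay hLay μ hμ u₀ hcode)

/-- **The contract of `residue_decode`**, from the unit `residue_decode`. -/
theorem ctr_residue_decode (L : Final.Leaves) (Lay : Layout) (hLay : Lay.hi = 0x1000000) (μ : Microarch) (hμ : UserX.MicroOK μ) (u₀ : State)
    (hcode : AllCode Lay u₀) :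
    ∀ (others : List Obj) (frames : List (Nat × FrameLayout)) (Blk : Block → Prop) (len : Nat), Calls Lay μ Vorbis.WayInv (Vorbis.conv u₀) Vorbis.L.residue_decode.entry (Vorbis.Spec.residue_decode.spec others frames Blk len) :=
  L.h_residue_decode Lay hLay μ hμ u₀ hcode.residue_decode
    (ctr_asan_load4_noabort L Lay hLay μ hμ u₀ hcode)
    (ctr_codebook_decode_step L Lay hLay μ hμ u₀ hcode)
    (ctr_codebook_decode L Lay hLay μ hμ u₀ hcode)

/-- Segment `decode_residue.1` of `decode_residue`: its claim, from the unit's statement. -/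
theorem seg_decode_residue_1 (L : Final.Leaves) (Lay : Layout) (hLay : Lay.hi = 0x1000000) (μ : Microarch) (hμ : UserX.MicroOK μ) (u₀ : State)
    (hcode : AllCode Lay u₀) :
    Vorbis.Spec.DecodeResidue.Seg1 Lay μ u₀ :=
  (stmt_decode_residue_1 L) Lay hLay μ hμ u₀ hcode.decode_residue
    (ctr_asan_load8_noabort L Lay hLay μ hμ u₀ hcode)
    (ctr_asan_load2_noabort L Lay hLay μ hμ u₀ hcode)
    (ctr_asan_load1_noabort L Lay hLay μ hμ u₀ hcode)
    (ctr_asan_load4_noabort L Lay hLay μ hμ u₀ hcode)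
    (ctr_setup_temp_malloc L Lay hLay μ hμ u₀ hcode)
    (ctr_make_block_array L Lay hLay μ hμ u₀ hcode)

/-- Segment `decode_residue.2` of `decode_residue`: its claim, from the unit's statement. -/
theorem seg_decode_residue_2 (L : Final.Leaves) (Lay : Layout) (hLay : Lay.hi = 0x1000000) (μ : Microarch) (hμ : UserX.MicroOK μ) (u₀ : State)
    (hcode : AllCode Lay u₀) :
    Vorbis.Spec.DecodeResidue.Seg2 Lay μ u₀ :=
  L.h_decode_residue_2 Lay hLay μ hμ u₀ hcode.decode_residue
    (ctr_asan_load1_noabort L Lay hLay μ hμ u₀ hcode)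
    (ctr_asan_load8_noabort L Lay hLay μ hμ u₀ hcode)
    (ctr_memset L Lay hLay μ hμ u₀ hcode)

/-- Segment `decode_residue.3` of `decode_residue`: its claim, from the unit's statement. -/
theorem seg_decode_residue_3 (L : Final.Leaves) (Lay : Layout) (hLay : Lay.hi = 0x1000000) (μ : Microarch) (hμ : UserX.MicroOK μ) (u₀ : State)
    (hcode : AllCode Lay u₀) :
    Vorbis.Spec.DecodeResidue.Seg3 Lay μ u₀ :=
  L.h_decode_residue_3 Lay hLay μ hμ u₀ hcode.decode_residue
    (ctr_asan_load1_noabort L Lay hLay μ hμ u₀ hcode)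

/-- Segment `decode_residue.4` of `decode_residue`: its claim, from the unit's statement. -/
theorem seg_decode_residue_4 (L : Final.Leaves) (Lay : Layout) (hLay : Lay.hi = 0x1000000) (μ : Microarch) (hμ : UserX.MicroOK μ) (u₀ : State)
    (hcode : AllCode Lay u₀) :
    Vorbis.Spec.DecodeResidue.Seg4 Lay μ u₀ :=
  (stmt_decode_residue_4 L) Lay hLay μ hμ u₀ hcode.decode_residue
    (ctr_asan_load8_noabort L Lay hLay μ hμ u₀ hcode)
    (ctr_codebook_decode_deinterleave_repeat L Lay hLay μ hμ u₀ hcode)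
    (ctr_asan_load4_noabort L Lay hLay μ hμ u₀ hcode)
    (ctr_asan_load1_noabort L Lay hLay μ hμ u₀ hcode)
    (ctr_asan_load2_noabort L Lay hLay μ hμ u₀ hcode)

/-- Segment `decode_residue.5` of `decode_residue`: its claim, from the unit's statement. -/
theorem seg_decode_residue_5 (L : Final.Leaves) (Lay : Layout) (hLay : Lay.hi = 0x1000000) (μ : Microarch) (hμ : UserX.MicroOK μ) (u₀ : State)
    (hcode : AllCode Lay u₀) :
    Vorbis.Spec.DecodeResidue.Seg5 Lay μ u₀ :=
  L.h_decode_residue_5 Lay hLay μ hμ u₀ hcode.decode_residue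
    (ctr_asan_load8_noabort L Lay hLay μ hμ u₀ hcode)
    (ctr_asan_load1_noabort L Lay hLay μ hμ u₀ hcode)
    (ctr_asan_load4_noabort L Lay hLay μ hμ u₀ hcode)
    (ctr_asan_load2_noabort L Lay hLay μ hμ u₀ hcode)
    (ctr_asan_store8_noabort L Lay hLay μ hμ u₀ hcode)
    (ctr_prep_huffman L Lay hLay μ hμ u₀ hcode)
    (ctr_codebook_decode_scalar_raw L Lay hLay μ hμ u₀ hcode)

/-- Segment `decode_residue.6` of `decode_residue`: its claim, from the unit's statement. -/
theorem seg_decode_residue_6 (L : Final.Leaves) (Lay : Layout) (hLay : Lay.hi = 0x1000000) (μ : Microarch) (hμ : UserX.MicroOK μ) (u₀ : State)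
    (hcode : AllCode Lay u₀) :
    Vorbis.Spec.DecodeResidue.Seg6 Lay μ u₀ :=
  (stmt_decode_residue_6 L) Lay hLay μ hμ u₀ hcode.decode_residue
    (ctr_asan_load8_noabort L Lay hLay μ hμ u₀ hcode)
    (ctr_codebook_decode_deinterleave_repeat L Lay hLay μ hμ u₀ hcode)
    (ctr_asan_load4_noabort L Lay hLay μ hμ u₀ hcode)
    (ctr_asan_load1_noabort L Lay hLay μ hμ u₀ hcode)
    (ctr_asan_load2_noabort L Lay hLay μ hμ u₀ hcode)

/-- Segment `decode_residue.7` of `decode_residue`: its claim, from the unit's statement. -/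
theorem seg_decode_residue_7 (L : Final.Leaves) (Lay : Layout) (hLay : Lay.hi = 0x1000000) (μ : Microarch) (hμ : UserX.MicroOK μ) (u₀ : State)
    (hcode : AllCode Lay u₀) :
    Vorbis.Spec.DecodeResidue.Seg7 Lay μ u₀ :=
  (stmt_decode_residue_7 L) Lay hLay μ hμ u₀ hcode.decode_residue
    (ctr_asan_load8_noabort L Lay hLay μ hμ u₀ hcode)
    (ctr_asan_load1_noabort L Lay hLay μ hμ u₀ hcode)
    (ctr_asan_load4_noabort L Lay hLay μ hμ u₀ hcode)
    (ctr_asan_load2_noabort L Lay hLay μ hμ u₀ hcode)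
    (ctr_asan_store8_noabort L Lay hLay μ hμ u₀ hcode)
    (ctr_prep_huffman L Lay hLay μ hμ u₀ hcode)
    (ctr_codebook_decode_scalar_raw L Lay hLay μ hμ u₀ hcode)

/-- Segment `decode_residue.8` of `decode_residue`: its claim, from the unit's statement. -/
theorem seg_decode_residue_8 (L : Final.Leaves) (Lay : Layout) (hLay : Lay.hi = 0x1000000) (μ : Microarch) (hμ : UserX.MicroOK μ) (u₀ : State)
    (hcode : AllCode Lay u₀) :
    Vorbis.Spec.DecodeResidue.Seg8 Lay μ u₀ :=
  L.h_decode_residue_8 Lay hLay μ hμ u₀ hcode.decode_residue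

/-- Segment `decode_residue.9` of `decode_residue`: its claim, from the unit's statement. -/
theorem seg_decode_residue_9 (L : Final.Leaves) (Lay : Layout) (hLay : Lay.hi = 0x1000000) (μ : Microarch) (hμ : UserX.MicroOK μ) (u₀ : State)
    (hcode : AllCode Lay u₀) :
    Vorbis.Spec.DecodeResidue.Seg9 Lay μ u₀ :=
  L.h_decode_residue_9 Lay hLay μ hμ u₀ hcode.decode_residue
    (ctr_prep_huffman L Lay hLay μ hμ u₀ hcode)
    (ctr_codebook_decode_scalar_raw L Lay hLay μ hμ u₀ hcode)
    (ctr_asan_load1_noabort L Lay hLay μ hμ u₀ hcode)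
    (ctr_asan_load8_noabort L Lay hLay μ hμ u₀ hcode)
    (ctr_asan_load4_noabort L Lay hLay μ hμ u₀ hcode)
    (ctr_asan_store8_noabort L Lay hLay μ hμ u₀ hcode)
    (ctr_asan_load2_noabort L Lay hLay μ hμ u₀ hcode)

/-- Segment `decode_residue.10` of `decode_residue`: its claim, from the unit's statement. -/
theorem seg_decode_residue_10 (L : Final.Leaves) (Lay : Layout) (hLay : Lay.hi = 0x1000000) (μ : Microarch) (hμ : UserX.MicroOK μ) (u₀ : State)
    (hcode : AllCode Lay u₀) :
    Vorbis.Spec.DecodeResidue.Seg10 Lay μ u₀ :=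
  L.h_decode_residue_10 Lay hLay μ hμ u₀ hcode.decode_residue
    (ctr_asan_load1_noabort L Lay hLay μ hμ u₀ hcode)
    (ctr_asan_load8_noabort L Lay hLay μ hμ u₀ hcode)
    (ctr_asan_load2_noabort L Lay hLay μ hμ u₀ hcode)
    (ctr_asan_load4_noabort L Lay hLay μ hμ u₀ hcode)
    (ctr_residue_decode L Lay hLay μ hμ u₀ hcode)

/-- Segment `decode_residue.11` of `decode_residue`: its claim, from the unit's statement. -/
theorem seg_decode_residue_11 (L : Final.Leaves) (Lay : Layout) (hLay : Lay.hi = 0x1000000) (μ : Microarch) (hμ : UserX.MicroOK μ) (u₀ : State)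
    (hcode : AllCode Lay u₀) :
    Vorbis.Spec.DecodeResidue.Seg11 Lay μ u₀ :=
  L.h_decode_residue_11 Lay hLay μ hμ u₀ hcode.decode_residue
    (ctr_arena_temp_restore L Lay hLay μ hμ u₀ hcode)

/-- **The contract of `decode_residue`**, from the composition of its segments (`decode_residue.COMPOSITION`). -/
theorem ctr_decode_residue (L : Final.Leaves) (Lay : Layout) (hLay : Lay.hi = 0x1000000) (μ : Microarch) (hμ : UserX.MicroOK μ) (u₀ : State)
    (hcode : AllCode Lay u₀) :
    ∀ (len : Nat) (A : Arena) (others : List Obj) (frames : List (Nat × FrameLayout)) (stored room : Int) (ysz : Nat → Nat), Calls Lay μ Vorbis.WayInv (Vorbis.conv u₀) Vorbis.L.decode_residue.entry (Vorbis.Spec.decode_residue.spec len A others frames stored room ysz) :=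
  Vorbis.Spec.Worked.decode_residue_COMPOSITION_ok Lay hLay μ hμ u₀
    (seg_decode_residue_1 L Lay hLay μ hμ u₀ hcode)
    (seg_decode_residue_2 L Lay hLay μ hμ u₀ hcode)
    (seg_decode_residue_3 L Lay hLay μ hμ u₀ hcode)
    (seg_decode_residue_4 L Lay hLay μ hμ u₀ hcode)
    (seg_decode_residue_5 L Lay hLay μ hμ u₀ hcode)
    (seg_decode_residue_6 L Lay hLay μ hμ u₀ hcode)
    (seg_decode_residue_7 L Lay hLay μ hμ u₀ hcode)
    (seg_decode_residue_8 L Lay hLay μ hμ u₀ hcode)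
    (seg_decode_residue_9 L Lay hLay μ hμ u₀ hcode)
    (seg_decode_residue_10 L Lay hLay μ hμ u₀ hcode)
    (seg_decode_residue_11 L Lay hLay μ hμ u₀ hcode)

/-- **The contract of `flush_packet`**, from the unit `flush_packet`. -/
theorem ctr_flush_packet (L : Final.Leaves) (Lay : Layout) (hLay : Lay.hi = 0x1000000) (μ : Microarch) (hμ : UserX.MicroOK μ) (u₀ : State)
    (hcode : AllCode Lay u₀) :
    ∀ (others : List Obj) (frames : List (Nat × FrameLayout)) (Blk : Block → Prop) (len : Nat), Calls Lay μ Vorbis.WayInv (Vorbis.conv u₀) Vorbis.L.flush_packet.entry (Vorbis.Spec.flush_packet.spec others frames Blk len) :=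
  L.h_flush_packet Lay hLay μ hμ u₀ hcode.flush_packet
    (ctr_get8_packet_raw L Lay hLay μ hμ u₀ hcode)

/-- Segment `vorbis_decode_packet_rest.1` of `vorbis_decode_packet_rest`: its claim, from the unit's statement. -/
theorem seg_vorbis_decode_packet_rest_1 (L : Final.Leaves) (Lay : Layout) (hLay : Lay.hi = 0x1000000) (μ : Microarch) (hμ : UserX.MicroOK μ) (u₀ : State)
    (hcode : AllCode Lay u₀) :
    Vorbis.Spec.vorbis_decode_packet_rest.Seg1 Lay μ u₀ :=
  (stmt_vorbis_decode_packet_rest_1 L) Lay hLay μ hμ u₀ hcode.vorbis_decode_packet_rest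
    (ctr_asan_load1_noabort L Lay hLay μ hμ u₀ hcode)
    (ctr_asan_load4_noabort L Lay hLay μ hμ u₀ hcode)
    (ctr_asan_load8_noabort L Lay hLay μ hμ u₀ hcode)

/-- Segment `vorbis_decode_packet_rest.2` of `vorbis_decode_packet_rest`: its claim, from the unit's statement. -/
theorem seg_vorbis_decode_packet_rest_2 (L : Final.Leaves) (Lay : Layout) (hLay : Lay.hi = 0x1000000) (μ : Microarch) (hμ : UserX.MicroOK μ) (u₀ : State)
    (hcode : AllCode Lay u₀) :
    Vorbis.Spec.vorbis_decode_packet_rest.Seg2 Lay μ u₀ :=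
  (stmt_vorbis_decode_packet_rest_2 L) Lay hLay μ hμ u₀ hcode.vorbis_decode_packet_rest
    (ctr_asan_load4_noabort L Lay hLay μ hμ u₀ hcode)
    (ctr_asan_load8_noabort L Lay hLay μ hμ u₀ hcode)
    (ctr_asan_load1_noabort L Lay hLay μ hμ u₀ hcode)
    (ctr_asan_store4_noabort L Lay hLay μ hμ u₀ hcode)
    (ctr_asan_load2_noabort L Lay hLay μ hμ u₀ hcode)
    (ctr_get_bits L Lay hLay μ hμ u₀ hcode)
    (ctr_ilog L Lay hLay μ hμ u₀ hcode)
    (ctr_asan_store2_noabort L Lay hLay μ hμ u₀ hcode)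

/-- Segment `vorbis_decode_packet_rest.3` of `vorbis_decode_packet_rest`: its claim, from the unit's statement. -/
theorem seg_vorbis_decode_packet_rest_3 (L : Final.Leaves) (Lay : Layout) (hLay : Lay.hi = 0x1000000) (μ : Microarch) (hμ : UserX.MicroOK μ) (u₀ : State)
    (hcode : AllCode Lay u₀) :
    Vorbis.Spec.vorbis_decode_packet_rest.Seg3 Lay μ u₀ :=
  (stmt_vorbis_decode_packet_rest_3 L) Lay hLay μ hμ u₀ hcode.vorbis_decode_packet_rest
    (ctr_prep_huffman L Lay hLay μ hμ u₀ hcode)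
    (ctr_codebook_decode_scalar_raw L Lay hLay μ hμ u₀ hcode)
    (ctr_asan_load1_noabort L Lay hLay μ hμ u₀ hcode)
    (ctr_asan_load8_noabort L Lay hLay μ hμ u₀ hcode)
    (ctr_asan_load4_noabort L Lay hLay μ hμ u₀ hcode)
    (ctr_asan_load2_noabort L Lay hLay μ hμ u₀ hcode)

/-- Segment `vorbis_decode_packet_rest.4` of `vorbis_decode_packet_rest`: its claim, from the unit's statement. -/
theorem seg_vorbis_decode_packet_rest_4 (L : Final.Leaves) (Lay : Layout) (hLay : Lay.hi = 0x1000000) (μ : Microarch) (hμ : UserX.MicroOK μ) (u₀ : State)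
    (hcode : AllCode Lay u₀) :
    Vorbis.Spec.vorbis_decode_packet_rest.Seg4 Lay μ u₀ :=
  (stmt_vorbis_decode_packet_rest_4 L) Lay hLay μ hμ u₀ hcode.vorbis_decode_packet_rest
    (ctr_prep_huffman L Lay hLay μ hμ u₀ hcode)
    (ctr_codebook_decode_scalar_raw L Lay hLay μ hμ u₀ hcode)
    (ctr_asan_load1_noabort L Lay hLay μ hμ u₀ hcode)
    (ctr_asan_load8_noabort L Lay hLay μ hμ u₀ hcode)
    (ctr_asan_load4_noabort L Lay hLay μ hμ u₀ hcode)
    (ctr_asan_store2_noabort L Lay hLay μ hμ u₀ hcode)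
    (ctr_asan_load2_noabort L Lay hLay μ hμ u₀ hcode)

/-- Segment `vorbis_decode_packet_rest.5` of `vorbis_decode_packet_rest`: its claim, from the unit's statement. -/
theorem seg_vorbis_decode_packet_rest_5 (L : Final.Leaves) (Lay : Layout) (hLay : Lay.hi = 0x1000000) (μ : Microarch) (hμ : UserX.MicroOK μ) (u₀ : State)
    (hcode : AllCode Lay u₀) :
    Vorbis.Spec.vorbis_decode_packet_rest.Seg5 Lay μ u₀ :=
  (stmt_vorbis_decode_packet_rest_5 L) Lay hLay μ hμ u₀ hcode.vorbis_decode_packet_rest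
    (ctr_asan_load4_noabort L Lay hLay μ hμ u₀ hcode)
    (ctr_asan_store1_noabort L Lay hLay μ hμ u₀ hcode)
    (ctr_asan_load1_noabort L Lay hLay μ hμ u₀ hcode)
    (ctr_asan_load2_noabort L Lay hLay μ hμ u₀ hcode)
    (ctr_predict_point L Lay hLay μ hμ u₀ hcode)

/-- Segment `vorbis_decode_packet_rest.6` of `vorbis_decode_packet_rest`: its claim, from the unit's statement. -/
theorem seg_vorbis_decode_packet_rest_6 (L : Final.Leaves) (Lay : Layout) (hLay : Lay.hi = 0x1000000) (μ : Microarch) (hμ : UserX.MicroOK μ) (u₀ : State)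
    (hcode : AllCode Lay u₀) :
    Vorbis.Spec.vorbis_decode_packet_rest.Seg6 Lay μ u₀ :=
  L.h_vorbis_decode_packet_rest_6 Lay hLay μ hμ u₀ hcode.vorbis_decode_packet_rest
    (ctr_asan_load1_noabort L Lay hLay μ hμ u₀ hcode)
    (ctr_asan_store2_noabort L Lay hLay μ hμ u₀ hcode)

/-- Segment `vorbis_decode_packet_rest.7` of `vorbis_decode_packet_rest`: its claim, from the unit's statement. -/
theorem seg_vorbis_decode_packet_rest_7 (L : Final.Leaves) (Lay : Layout) (hLay : Lay.hi = 0x1000000) (μ : Microarch) (hμ : UserX.MicroOK μ) (u₀ : State)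
    (hcode : AllCode Lay u₀) :
    Vorbis.Spec.vorbis_decode_packet_rest.Seg7 Lay μ u₀ :=
  L.h_vorbis_decode_packet_rest_7 Lay hLay μ hμ u₀ hcode.vorbis_decode_packet_rest
    (ctr_asan_store4_noabort L Lay hLay μ hμ u₀ hcode)

/-- Segment `vorbis_decode_packet_rest.8` of `vorbis_decode_packet_rest`: its claim, from the unit's statement. -/
theorem seg_vorbis_decode_packet_rest_8 (L : Final.Leaves) (Lay : Layout) (hLay : Lay.hi = 0x1000000) (μ : Microarch) (hμ : UserX.MicroOK μ) (u₀ : State)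
    (hcode : AllCode Lay u₀) :
    Vorbis.Spec.vorbis_decode_packet_rest.Seg8 Lay μ u₀ :=
  L.h_vorbis_decode_packet_rest_8 Lay hLay μ hμ u₀ hcode.vorbis_decode_packet_rest
    (ctr_memcpy L Lay hLay μ hμ u₀ hcode)
    (ctr_asan_load1_noabort L Lay hLay μ hμ u₀ hcode)
    (ctr_asan_store4_noabort L Lay hLay μ hμ u₀ hcode)
    (ctr_asan_load2_noabort L Lay hLay μ hμ u₀ hcode)
    (ctr_asan_load8_noabort L Lay hLay μ hμ u₀ hcode)
    (ctr_asan_load4_noabort L Lay hLay μ hμ u₀ hcode)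

/-- Segment `vorbis_decode_packet_rest.9` of `vorbis_decode_packet_rest`: its claim, from the unit's statement. -/
theorem seg_vorbis_decode_packet_rest_9 (L : Final.Leaves) (Lay : Layout) (hLay : Lay.hi = 0x1000000) (μ : Microarch) (hμ : UserX.MicroOK μ) (u₀ : State)
    (hcode : AllCode Lay u₀) :
    Vorbis.Spec.vorbis_decode_packet_rest.Seg9 Lay μ u₀ :=
  L.h_vorbis_decode_packet_rest_9 Lay hLay μ hμ u₀ hcode.vorbis_decode_packet_rest
    (ctr_asan_store1_noabort L Lay hLay μ hμ u₀ hcode)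
    (ctr_asan_load8_noabort L Lay hLay μ hμ u₀ hcode)
    (ctr_asan_store8_noabort L Lay hLay μ hμ u₀ hcode)
    (ctr_asan_load4_noabort L Lay hLay μ hμ u₀ hcode)
    (ctr_asan_load1_noabort L Lay hLay μ hμ u₀ hcode)
    (ctr_decode_residue L Lay hLay μ hμ u₀ hcode)

/-- Segment `vorbis_decode_packet_rest.10` of `vorbis_decode_packet_rest`: its claim, from the unit's statement. -/
theorem seg_vorbis_decode_packet_rest_10 (L : Final.Leaves) (Lay : Layout) (hLay : Lay.hi = 0x1000000) (μ : Microarch) (hμ : UserX.MicroOK μ) (u₀ : State)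
    (hcode : AllCode Lay u₀) :
    Vorbis.Spec.vorbis_decode_packet_rest.Seg10 Lay μ u₀ :=
  L.h_vorbis_decode_packet_rest_10 Lay hLay μ hμ u₀ hcode.vorbis_decode_packet_rest
    (ctr_asan_load2_noabort L Lay hLay μ hμ u₀ hcode)
    (ctr_asan_store4_noabort L Lay hLay μ hμ u₀ hcode)
    (ctr_asan_load4_noabort L Lay hLay μ hμ u₀ hcode)
    (ctr_asan_load8_noabort L Lay hLay μ hμ u₀ hcode)
    (ctr_asan_load1_noabort L Lay hLay μ hμ u₀ hcode)

/-- Segment `vorbis_decode_packet_rest.11` of `vorbis_decode_packet_rest`: its claim, from the unit's statement. -/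
theorem seg_vorbis_decode_packet_rest_11 (L : Final.Leaves) (Lay : Layout) (hLay : Lay.hi = 0x1000000) (μ : Microarch) (hμ : UserX.MicroOK μ) (u₀ : State)
    (hcode : AllCode Lay u₀) :
    Vorbis.Spec.vorbis_decode_packet_rest.Seg11 Lay μ u₀ :=
  L.h_vorbis_decode_packet_rest_11 Lay hLay μ hμ u₀ hcode.vorbis_decode_packet_rest
    (ctr_asan_load8_noabort L Lay hLay μ hμ u₀ hcode)
    (ctr_do_floor L Lay hLay μ hμ u₀ hcode)
    (ctr_asan_load4_noabort L Lay hLay μ hμ u₀ hcode)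
    (ctr_memset L Lay hLay μ hμ u₀ hcode)

/-- Segment `vorbis_decode_packet_rest.12` of `vorbis_decode_packet_rest`: its claim, from the unit's statement. -/
theorem seg_vorbis_decode_packet_rest_12 (L : Final.Leaves) (Lay : Layout) (hLay : Lay.hi = 0x1000000) (μ : Microarch) (hμ : UserX.MicroOK μ) (u₀ : State)
    (hcode : AllCode Lay u₀) :
    Vorbis.Spec.vorbis_decode_packet_rest.Seg12 Lay μ u₀ :=
  L.h_vorbis_decode_packet_rest_12 Lay hLay μ hμ u₀ hcode.vorbis_decode_packet_rest
    (ctr_asan_load1_noabort L Lay hLay μ hμ u₀ hcode)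
    (ctr_asan_load8_noabort L Lay hLay μ hμ u₀ hcode)
    (ctr_inverse_mdct L Lay hLay μ hμ u₀ hcode)
    (ctr_asan_load4_noabort L Lay hLay μ hμ u₀ hcode)

/-- Segment `vorbis_decode_packet_rest.13` of `vorbis_decode_packet_rest`: its claim, from the unit's statement. -/
theorem seg_vorbis_decode_packet_rest_13 (L : Final.Leaves) (Lay : Layout) (hLay : Lay.hi = 0x1000000) (μ : Microarch) (hμ : UserX.MicroOK μ) (u₀ : State)
    (hcode : AllCode Lay u₀) :
    Vorbis.Spec.vorbis_decode_packet_rest.Seg13 Lay μ u₀ :=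
  L.h_vorbis_decode_packet_rest_13 Lay hLay μ hμ u₀ hcode.vorbis_decode_packet_rest
    (ctr_flush_packet L Lay hLay μ hμ u₀ hcode)
    (ctr_asan_load1_noabort L Lay hLay μ hμ u₀ hcode)
    (ctr_asan_store4_noabort L Lay hLay μ hμ u₀ hcode)
    (ctr_asan_load4_noabort L Lay hLay μ hμ u₀ hcode)

/-- Segment `vorbis_decode_packet_rest.14` of `vorbis_decode_packet_rest`: its claim, from the unit's statement. -/
theorem seg_vorbis_decode_packet_rest_14 (L : Final.Leaves) (Lay : Layout) (hLay : Lay.hi = 0x1000000) (μ : Microarch) (hμ : UserX.MicroOK μ) (u₀ : State)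
    (hcode : AllCode Lay u₀) :
    Vorbis.Spec.vorbis_decode_packet_rest.Seg14 Lay μ u₀ :=
  L.h_vorbis_decode_packet_rest_14 Lay hLay μ hμ u₀ hcode.vorbis_decode_packet_rest
    (ctr_asan_load4_noabort L Lay hLay μ hμ u₀ hcode)
    (ctr_asan_store4_noabort L Lay hLay μ hμ u₀ hcode)
    (ctr_asan_load1_noabort L Lay hLay μ hμ u₀ hcode)

/-- Segment `vorbis_decode_packet_rest.15` of `vorbis_decode_packet_rest`: its claim, from the unit's statement. -/
theorem seg_vorbis_decode_packet_rest_15 (L : Final.Leaves) (Lay : Layout) (hLay : Lay.hi = 0x1000000) (μ : Microarch) (hμ : UserX.MicroOK μ) (u₀ : State)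
    (hcode : AllCode Lay u₀) :
    Vorbis.Spec.vorbis_decode_packet_rest.Seg15 Lay μ u₀ :=
  L.h_vorbis_decode_packet_rest_15 Lay hLay μ hμ u₀ hcode.vorbis_decode_packet_rest

/-- Segment `vorbis_decode_packet_rest.16` of `vorbis_decode_packet_rest`: its claim, from the unit's statement. -/
theorem seg_vorbis_decode_packet_rest_16 (L : Final.Leaves) (Lay : Layout) (hLay : Lay.hi = 0x1000000) (μ : Microarch) (hμ : UserX.MicroOK μ) (u₀ : State)
    (hcode : AllCode Lay u₀) :
    Vorbis.Spec.vorbis_decode_packet_rest.Seg16 Lay μ u₀ :=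
  L.h_vorbis_decode_packet_rest_16 Lay hLay μ hμ u₀ hcode.vorbis_decode_packet_rest
    (ctr_error L Lay hLay μ hμ u₀ hcode)

/-- **The contract of `vorbis_decode_packet_rest`**, from the composition of its segments (`vorbis_decode_packet_rest.COMPOSITION`). -/
theorem ctr_vorbis_decode_packet_rest (L : Final.Leaves) (Lay : Layout) (hLay : Lay.hi = 0x1000000) (μ : Microarch) (hμ : UserX.MicroOK μ) (u₀ : State)
    (hcode : AllCode Lay u₀) :
    ∀ (others : List Obj) (frames : List (Nat × FrameLayout)) (len : Nat) (Ar : Arena) (stored room : Int) (mode : Nat) (ysz : Nat → Nat), Calls Lay μ Vorbis.WayInv (Vorbis.conv u₀) Vorbis.L.vorbis_decode_packet_rest.entry (Vorbis.Spec.vorbis_decode_packet_rest.spec others frames len Ar stored room mode ysz) :=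
  Vorbis.Spec.Worked.vorbis_decode_packet_rest_COMPOSITION_ok Lay hLay μ hμ u₀
    (seg_vorbis_decode_packet_rest_1 L Lay hLay μ hμ u₀ hcode)
    (seg_vorbis_decode_packet_rest_2 L Lay hLay μ hμ u₀ hcode)
    (seg_vorbis_decode_packet_rest_3 L Lay hLay μ hμ u₀ hcode)
    (seg_vorbis_decode_packet_rest_4 L Lay hLay μ hμ u₀ hcode)
    (seg_vorbis_decode_packet_rest_5 L Lay hLay μ hμ u₀ hcode)
    (seg_vorbis_decode_packet_rest_6 L Lay hLay μ hμ u₀ hcode)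
    (seg_vorbis_decode_packet_rest_7 L Lay hLay μ hμ u₀ hcode)
    (seg_vorbis_decode_packet_rest_8 L Lay hLay μ hμ u₀ hcode)
    (seg_vorbis_decode_packet_rest_9 L Lay hLay μ hμ u₀ hcode)
    (seg_vorbis_decode_packet_rest_10 L Lay hLay μ hμ u₀ hcode)
    (seg_vorbis_decode_packet_rest_11 L Lay hLay μ hμ u₀ hcode)
    (seg_vorbis_decode_packet_rest_12 L Lay hLay μ hμ u₀ hcode)
    (seg_vorbis_decode_packet_rest_13 L Lay hLay μ hμ u₀ hcode)
    (seg_vorbis_decode_packet_rest_14 L Lay hLay μ hμ u₀ hcode)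
    (seg_vorbis_decode_packet_rest_15 L Lay hLay μ hμ u₀ hcode)
    (seg_vorbis_decode_packet_rest_16 L Lay hLay μ hμ u₀ hcode)

/-- **The contract of `get8_packet`**, from the unit `get8_packet`. -/
theorem ctr_get8_packet (L : Final.Leaves) (Lay : Layout) (hLay : Lay.hi = 0x1000000) (μ : Microarch) (hμ : UserX.MicroOK μ) (u₀ : State)
    (hcode : AllCode Lay u₀) :
    ∀ (others : List Obj) (frames : List (Nat × FrameLayout)) (Blk : Block → Prop) (len : Nat), Calls Lay μ Vorbis.WayInv (Vorbis.conv u₀) Vorbis.L.get8_packet.entry (Vorbis.Spec.get8_packet.spec others frames Blk len) :=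
  L.h_get8_packet Lay hLay μ hμ u₀ hcode.get8_packet
    (ctr_get8_packet_raw L Lay hLay μ hμ u₀ hcode)
    (ctr_asan_store4_noabort L Lay hLay μ hμ u₀ hcode)

/-- **The contract of `start_packet`**, from the unit `start_packet`. -/
theorem ctr_start_packet (L : Final.Leaves) (Lay : Layout) (hLay : Lay.hi = 0x1000000) (μ : Microarch) (hμ : UserX.MicroOK μ) (u₀ : State)
    (hcode : AllCode Lay u₀) :
    ∀ (others : List Obj) (frames : List (Nat × FrameLayout)) (Blk : Block → Prop) (len : Nat), Calls Lay μ Vorbis.WayInv (Vorbis.conv u₀) Vorbis.L.start_packet.entry (Vorbis.Spec.start_packet.spec others frames Blk len) :=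
  L.h_start_packet Lay hLay μ hμ u₀ hcode.start_packet
    (ctr_asan_load4_noabort L Lay hLay μ hμ u₀ hcode)
    (ctr_start_page L Lay hLay μ hμ u₀ hcode)
    (ctr_asan_load1_noabort L Lay hLay μ hμ u₀ hcode)
    (ctr_error L Lay hLay μ hμ u₀ hcode)
    (ctr_asan_store4_noabort L Lay hLay μ hμ u₀ hcode)
    (ctr_asan_store1_noabort L Lay hLay μ hμ u₀ hcode)

/-- **The contract of `maybe_start_packet`**, from the unit `maybe_start_packet`. -/
theorem ctr_maybe_start_packet (L : Final.Leaves) (Lay : Layout) (hLay : Lay.hi = 0x1000000) (μ : Microarch) (hμ : UserX.MicroOK μ) (u₀ : State)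
    (hcode : AllCode Lay u₀) :
    ∀ (others : List Obj) (frames : List (Nat × FrameLayout)) (Blk : Block → Prop) (len : Nat), Calls Lay μ Vorbis.WayInv (Vorbis.conv u₀) Vorbis.L.maybe_start_packet.entry (Vorbis.Spec.maybe_start_packet.spec others frames Blk len) :=
  L.h_maybe_start_packet Lay hLay μ hμ u₀ hcode.maybe_start_packet
    (ctr_asan_load4_noabort L Lay hLay μ hμ u₀ hcode)
    (ctr_start_packet L Lay hLay μ hμ u₀ hcode)
    (ctr_get8 L Lay hLay μ hμ u₀ hcode)
    (ctr_error L Lay hLay μ hμ u₀ hcode)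
    (ctr_start_page_no_capturepattern L Lay hLay μ hμ u₀ hcode)
    (ctr_asan_load1_noabort L Lay hLay μ hμ u₀ hcode)
    (ctr_asan_store4_noabort L Lay hLay μ hμ u₀ hcode)
    (ctr_asan_store1_noabort L Lay hLay μ hμ u₀ hcode)

/-- **The contract of `vorbis_decode_initial`**, from the unit `vorbis_decode_initial`. -/
theorem ctr_vorbis_decode_initial (L : Final.Leaves) (Lay : Layout) (hLay : Lay.hi = 0x1000000) (μ : Microarch) (hμ : UserX.MicroOK μ) (u₀ : State)
    (hcode : AllCode Lay u₀) :
    ∀ (others : List Obj) (frames : List (Nat × FrameLayout)) (len : Nat) (A : Arena) (stored room : Int) (ysz : Nat → Nat), Calls Lay μ Vorbis.WayInv (Vorbis.conv u₀) Vorbis.L.vorbis_decode_initial.entry (Vorbis.Spec.vorbis_decode_initial.spec others frames len A stored room ysz) :=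
  (stmt_vorbis_decode_initial L) Lay hLay μ hμ u₀ hcode.vorbis_decode_initial
    (ctr_asan_store4_noabort L Lay hLay μ hμ u₀ hcode)
    (ctr_asan_load4_noabort L Lay hLay μ hμ u₀ hcode)
    (ctr_maybe_start_packet L Lay hLay μ hμ u₀ hcode)
    (ctr_get_bits L Lay hLay μ hμ u₀ hcode)
    (ctr_get8_packet L Lay hLay μ hμ u₀ hcode)
    (ctr_ilog L Lay hLay μ hμ u₀ hcode)
    (ctr_asan_load1_noabort L Lay hLay μ hμ u₀ hcode)

/-- **The contract of `vorbis_decode_packet`**, from the unit `vorbis_decode_packet`. -/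
theorem ctr_vorbis_decode_packet (L : Final.Leaves) (Lay : Layout) (hLay : Lay.hi = 0x1000000) (μ : Microarch) (hμ : UserX.MicroOK μ) (u₀ : State)
    (hcode : AllCode Lay u₀) :
    ∀ (others : List Obj) (frames : List (Nat × FrameLayout)) (len : Nat) (A : Arena) (stored room : Int) (ysz : Nat → Nat), Calls Lay μ Vorbis.WayInv (Vorbis.conv u₀) Vorbis.L.vorbis_decode_packet.entry (Vorbis.Spec.vorbis_decode_packet.spec others frames len A stored room ysz) :=
  L.h_vorbis_decode_packet Lay hLay μ hμ u₀ hcode.vorbis_decode_packet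
    (ctr_vorbis_decode_initial L Lay hLay μ hμ u₀ hcode)
    (ctr_asan_load4_noabort L Lay hLay μ hμ u₀ hcode)
    (ctr_vorbis_decode_packet_rest L Lay hLay μ hμ u₀ hcode)

/-- **The contract of `stb_vorbis_get_frame_float`**, from the unit `stb_vorbis_get_frame_float`. -/
theorem ctr_stb_vorbis_get_frame_float (L : Final.Leaves) (Lay : Layout) (hLay : Lay.hi = 0x1000000) (μ : Microarch) (hμ : UserX.MicroOK μ) (u₀ : State)
    (hcode : AllCode Lay u₀) :
    ∀ (others : List Obj) (frames : List (Nat × FrameLayout)) (len : Nat) (A : Arena) (stored room : Int) (ysz : Nat → Nat), Calls Lay μ Vorbis.WayInv (Vorbis.conv u₀) Vorbis.L.stb_vorbis_get_frame_float.entry (Vorbis.Spec.stb_vorbis_get_frame_float.spec others frames len A stored room ysz) :=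
  (stmt_stb_vorbis_get_frame_float L) Lay hLay μ hμ u₀ hcode.stb_vorbis_get_frame_float
    (ctr_vorbis_decode_packet L Lay hLay μ hμ u₀ hcode)
    (ctr_asan_store4_noabort L Lay hLay μ hμ u₀ hcode)
    (ctr_vorbis_finish_frame L Lay hLay μ hμ u₀ hcode)
    (ctr_asan_load8_noabort L Lay hLay μ hμ u₀ hcode)
    (ctr_asan_store8_noabort L Lay hLay μ hμ u₀ hcode)
    (ctr_asan_load4_noabort L Lay hLay μ hμ u₀ hcode)

/-- **The contract of `range_bad`**, from the unit `range_bad`. -/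
theorem ctr_range_bad (L : Final.Leaves) (Lay : Layout) (hLay : Lay.hi = 0x1000000) (μ : Microarch) (hμ : UserX.MicroOK μ) (u₀ : State)
    (hcode : AllCode Lay u₀) :
    Calls Lay μ Vorbis.WayInv (Vorbis.conv u₀) Vorbis.L.range_bad.entry Asan.rangeBadSpec :=
  L.h_range_bad Lay hLay μ hμ u₀ hcode.range_bad

/-- **The contract of `__asan_storeN_noabort`**, from the unit `__asan_storeN_noabort`. -/
theorem ctr_asan_storeN_noabort (L : Final.Leaves) (Lay : Layout) (hLay : Lay.hi = 0x1000000) (μ : Microarch) (hμ : UserX.MicroOK μ) (u₀ : State)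
    (hcode : AllCode Lay u₀) :
    Calls Lay μ Vorbis.WayInv (Vorbis.conv u₀) Vorbis.L.__asan_storeN_noabort.entry Asan.checkNSpec :=
  L.h_asan_storeN_noabort Lay hLay μ hμ u₀ hcode.asan_storeN_noabort
    (ctr_range_bad L Lay hLay μ hμ u₀ hcode)

/-- **The contract of `__asan_load16_noabort`**, from the unit `__asan_load16_noabort`. -/
theorem ctr_asan_load16_noabort (L : Final.Leaves) (Lay : Layout) (hLay : Lay.hi = 0x1000000) (μ : Microarch) (hμ : UserX.MicroOK μ) (u₀ : State)
    (hcode : AllCode Lay u₀) :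
    Calls Lay μ Vorbis.WayInv (Vorbis.conv u₀) Vorbis.L.__asan_load16_noabort.entry Asan.check16Spec :=
  L.h_asan_load16_noabort Lay hLay μ hμ u₀ hcode.asan_load16_noabort
    (ctr_range_bad L Lay hLay μ hμ u₀ hcode)

/-- **The contract of `__asan_store16_noabort`**, from the unit `__asan_store16_noabort`. -/
theorem ctr_asan_store16_noabort (L : Final.Leaves) (Lay : Layout) (hLay : Lay.hi = 0x1000000) (μ : Microarch) (hμ : UserX.MicroOK μ) (u₀ : State)
    (hcode : AllCode Lay u₀) :
    Calls Lay μ Vorbis.WayInv (Vorbis.conv u₀) Vorbis.L.__asan_store16_noabort.entry Asan.check16Spec :=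
  L.h_asan_store16_noabort Lay hLay μ hμ u₀ hcode.asan_store16_noabort
    (ctr_range_bad L Lay hLay μ hμ u₀ hcode)

/-- **The contract of `vorbis_init`**, from the unit `vorbis_init`. -/
theorem ctr_vorbis_init (L : Final.Leaves) (Lay : Layout) (hLay : Lay.hi = 0x1000000) (μ : Microarch) (hμ : UserX.MicroOK μ) (u₀ : State)
    (hcode : AllCode Lay u₀) :
    ∀ (others : List Obj) (frames : List (Nat × FrameLayout)) (B len : Nat), Calls Lay μ Vorbis.WayInv (Vorbis.conv u₀) Vorbis.L.vorbis_init.entry (Vorbis.Spec.vorbis_init.spec others frames B len) :=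
  L.h_vorbis_init Lay hLay μ hμ u₀ hcode.vorbis_init
    (ctr_memset L Lay hLay μ hμ u₀ hcode)
    (ctr_asan_store16_noabort L Lay hLay μ hμ u₀ hcode)
    (ctr_asan_load16_noabort L Lay hLay μ hμ u₀ hcode)
    (ctr_asan_load4_noabort L Lay hLay μ hμ u₀ hcode)
    (ctr_asan_store4_noabort L Lay hLay μ hμ u₀ hcode)
    (ctr_asan_store8_noabort L Lay hLay μ hμ u₀ hcode)

/-- **The contract of `setup_malloc`**, from the unit `setup_malloc`. -/
theorem ctr_setup_malloc (L : Final.Leaves) (Lay : Layout) (hLay : Lay.hi = 0x1000000) (μ : Microarch) (hμ : UserX.MicroOK μ) (u₀ : State)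
    (hcode : AllCode Lay u₀) :
    ∀ (others : List Obj) (frames : List (Nat × FrameLayout)) (A : Arena), Calls Lay μ Vorbis.WayInv (Vorbis.conv u₀) Vorbis.L.setup_malloc.entry (Vorbis.Spec.setup_malloc.spec others frames A) :=
  L.h_setup_malloc Lay hLay μ hμ u₀ hcode.setup_malloc
    (ctr_asan_load8_noabort L Lay hLay μ hμ u₀ hcode)
    (ctr_asan_load4_noabort L Lay hLay μ hμ u₀ hcode)
    (ctr_arena_unpoison L Lay hLay μ hμ u₀ hcode)
    (ctr_malloc L Lay hLay μ hμ u₀ hcode)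

/-- **The contract of `vorbis_alloc`**, from the unit `vorbis_alloc`. -/
theorem ctr_vorbis_alloc (L : Final.Leaves) (Lay : Layout) (hLay : Lay.hi = 0x1000000) (μ : Microarch) (hμ : UserX.MicroOK μ) (u₀ : State)
    (hcode : AllCode Lay u₀) :
    ∀ (others : List Obj) (frames : List (Nat × FrameLayout)) (A : Arena), Calls Lay μ Vorbis.WayInv (Vorbis.conv u₀) Vorbis.L.vorbis_alloc.entry (Vorbis.Spec.vorbis_alloc.spec others frames A) :=
  L.h_vorbis_alloc Lay hLay μ hμ u₀ hcode.vorbis_alloc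
    (ctr_setup_malloc L Lay hLay μ hμ u₀ hcode)

/-- **The contract of `vorbis_pump_first_frame`**, from the unit `vorbis_pump_first_frame`. -/
theorem ctr_vorbis_pump_first_frame (L : Final.Leaves) (Lay : Layout) (hLay : Lay.hi = 0x1000000) (μ : Microarch) (hμ : UserX.MicroOK μ) (u₀ : State)
    (hcode : AllCode Lay u₀) :
    ∀ (others : List Obj) (frames : List (Nat × FrameLayout)) (len : Nat) (A : Arena) (stored room : Int) (ysz : Nat → Nat), Calls Lay μ Vorbis.WayInv (Vorbis.conv u₀) Vorbis.L.vorbis_pump_first_frame.entry (Vorbis.Spec.vorbis_pump_first_frame.spec others frames len A stored room ysz) :=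
  L.h_vorbis_pump_first_frame Lay hLay μ hμ u₀ hcode.vorbis_pump_first_frame
    (ctr_vorbis_decode_packet L Lay hLay μ hμ u₀ hcode)
    (ctr_vorbis_finish_frame L Lay hLay μ hμ u₀ hcode)

/-- **The contract of `swap_bytes`**, from the unit `swap_bytes`. -/
theorem ctr_swap_bytes (L : Final.Leaves) (Lay : Layout) (hLay : Lay.hi = 0x1000000) (μ : Microarch) (hμ : UserX.MicroOK μ) (u₀ : State)
    (hcode : AllCode Lay u₀) :
    ∀ (others : List Obj) (frames : List (Nat × FrameLayout)), Calls Lay μ Vorbis.WayInv (Vorbis.conv u₀) Vorbis.L.swap_bytes.entry (Vorbis.Spec.swap_bytes.spec others frames) :=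
  L.h_swap_bytes Lay hLay μ hμ u₀ hcode.swap_bytes
    (ctr_asan_load1_noabort L Lay hLay μ hμ u₀ hcode)

/-- **The contract of `uint32_compare`**, from the unit `uint32_compare`. -/
theorem ctr_uint32_compare (L : Final.Leaves) (Lay : Layout) (hLay : Lay.hi = 0x1000000) (μ : Microarch) (hμ : UserX.MicroOK μ) (u₀ : State)
    (hcode : AllCode Lay u₀) :
    ∀ (others : List Obj) (frames : List (Nat × FrameLayout)), Calls Lay μ Vorbis.WayInv (Vorbis.conv u₀) Vorbis.L.uint32_compare.entry (Vorbis.Spec.uint32_compare.spec others frames) :=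
  L.h_uint32_compare Lay hLay μ hμ u₀ hcode.uint32_compare
    (ctr_asan_load4_noabort L Lay hLay μ hμ u₀ hcode)

/-- **The contract of `point_compare`**, from the unit `point_compare`. -/
theorem ctr_point_compare (L : Final.Leaves) (Lay : Layout) (hLay : Lay.hi = 0x1000000) (μ : Microarch) (hμ : UserX.MicroOK μ) (u₀ : State)
    (hcode : AllCode Lay u₀) :
    ∀ (others : List Obj) (frames : List (Nat × FrameLayout)), Calls Lay μ Vorbis.WayInv (Vorbis.conv u₀) Vorbis.L.point_compare.entry (Vorbis.Spec.point_compare.spec others frames) :=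
  L.h_point_compare Lay hLay μ hμ u₀ hcode.point_compare
    (ctr_asan_load2_noabort L Lay hLay μ hμ u₀ hcode)

/-- **The contract of `sift_down`**, from the unit `sift_down`. -/
theorem ctr_sift_down (L : Final.Leaves) (Lay : Layout) (hLay : Lay.hi = 0x1000000) (μ : Microarch) (hμ : UserX.MicroOK μ) (u₀ : State)
    (hcode : AllCode Lay u₀) :
    ∀ (others : List Obj) (frames : List (Nat × FrameLayout)) (cmp : Word) (w : Nat), Vorbis.Spec.CmpSpec Lay μ u₀ others frames cmp w → Calls Lay μ Vorbis.WayInv (Vorbis.conv u₀) Vorbis.L.sift_down.entry (Vorbis.Spec.sift_down.spec others frames cmp w) :=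
  L.h_sift_down Lay hLay μ hμ u₀ hcode.sift_down
    (ctr_swap_bytes L Lay hLay μ hμ u₀ hcode)

/-- **The contract of `qsort`**, from the unit `qsort`. -/
theorem ctr_qsort (L : Final.Leaves) (Lay : Layout) (hLay : Lay.hi = 0x1000000) (μ : Microarch) (hμ : UserX.MicroOK μ) (u₀ : State)
    (hcode : AllCode Lay u₀) :
    ∀ (others : List Obj) (frames : List (Nat × FrameLayout)) (cmp : Word) (w : Nat), Vorbis.Spec.CmpSpec Lay μ u₀ others frames cmp w → Calls Lay μ Vorbis.WayInv (Vorbis.conv u₀) Vorbis.L.qsort.entry (Vorbis.Spec.qsort.spec others frames cmp w) :=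
  L.h_qsort Lay hLay μ hμ u₀ hcode.qsort
    (ctr_sift_down L Lay hLay μ hμ u₀ hcode)
    (ctr_swap_bytes L Lay hLay μ hμ u₀ hcode)

/-- **The contract of `crc32_init`**, from the unit `crc32_init`. -/
theorem ctr_crc32_init (L : Final.Leaves) (Lay : Layout) (hLay : Lay.hi = 0x1000000) (μ : Microarch) (hμ : UserX.MicroOK μ) (u₀ : State)
    (hcode : AllCode Lay u₀) :
    ∀ (others : List Obj) (frames : List (Nat × FrameLayout)), Calls Lay μ Vorbis.WayInv (Vorbis.conv u₀) Vorbis.L.crc32_init.entry (Vorbis.Spec.crc32_init.spec others frames) :=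
  L.h_crc32_init Lay hLay μ hμ u₀ hcode.crc32_init
    (ctr_asan_store4_noabort L Lay hLay μ hμ u₀ hcode)

/-- **The contract of `compute_accelerated_huffman`**, from the unit `compute_accelerated_huffman`. -/
theorem ctr_compute_accelerated_huffman (L : Final.Leaves) (Lay : Layout) (hLay : Lay.hi = 0x1000000) (μ : Microarch) (hμ : UserX.MicroOK μ) (u₀ : State)
    (hcode : AllCode Lay u₀) :
    ∀ (others : List Obj) (frames : List (Nat × FrameLayout)) (Blk : Block → Prop), Calls Lay μ Vorbis.WayInv (Vorbis.conv u₀) Vorbis.L.compute_accelerated_huffman.entry (Vorbis.Spec.compute_accelerated_huffman.spec others frames Blk) :=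
  L.h_compute_accelerated_huffman Lay hLay μ hμ u₀ hcode.compute_accelerated_huffman
    (ctr_asan_store2_noabort L Lay hLay μ hμ u₀ hcode)
    (ctr_asan_load1_noabort L Lay hLay μ hμ u₀ hcode)
    (ctr_asan_load4_noabort L Lay hLay μ hμ u₀ hcode)
    (ctr_asan_load8_noabort L Lay hLay μ hμ u₀ hcode)
    (ctr_bit_reverse L Lay hLay μ hμ u₀ hcode)

/-- **The contract of `neighbors`**, from the unit `neighbors`. -/
theorem ctr_neighbors (L : Final.Leaves) (Lay : Layout) (hLay : Lay.hi = 0x1000000) (μ : Microarch) (hμ : UserX.MicroOK μ) (u₀ : State)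
    (hcode : AllCode Lay u₀) :
    ∀ (others : List Obj) (frames : List (Nat × FrameLayout)), Calls Lay μ Vorbis.WayInv (Vorbis.conv u₀) Vorbis.L.neighbors.entry (Vorbis.Spec.neighbors.spec others frames) :=
  L.h_neighbors Lay hLay μ hμ u₀ hcode.neighbors
    (ctr_asan_load2_noabort L Lay hLay μ hμ u₀ hcode)
    (ctr_asan_store4_noabort L Lay hLay μ hμ u₀ hcode)

/-- **The contract of `skip`**, from the unit `skip`. -/
theorem ctr_skip (L : Final.Leaves) (Lay : Layout) (hLay : Lay.hi = 0x1000000) (μ : Microarch) (hμ : UserX.MicroOK μ) (u₀ : State)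
    (hcode : AllCode Lay u₀) :
    ∀ (others : List Obj) (frames : List (Nat × FrameLayout)) (Blk : Block → Prop) (len : Nat), Calls Lay μ Vorbis.WayInv (Vorbis.conv u₀) Vorbis.L.skip.entry (Vorbis.Spec.skip.spec others frames Blk len) :=
  L.h_skip Lay hLay μ hμ u₀ hcode.skip
    (ctr_asan_load8_noabort L Lay hLay μ hμ u₀ hcode)
    (ctr_asan_store4_noabort L Lay hLay μ hμ u₀ hcode)

/-- **The contract of `add_entry`**, from the unit `add_entry`. -/
theorem ctr_add_entry (L : Final.Leaves) (Lay : Layout) (hLay : Lay.hi = 0x1000000) (μ : Microarch) (hμ : UserX.MicroOK μ) (u₀ : State)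
    (hcode : AllCode Lay u₀) :
    ∀ (others : List Obj) (frames : List (Nat × FrameLayout)), Calls Lay μ Vorbis.WayInv (Vorbis.conv u₀) Vorbis.L.add_entry.entry (Vorbis.Spec.add_entry.spec others frames) :=
  L.h_add_entry Lay hLay μ hμ u₀ hcode.add_entry
    (ctr_asan_load1_noabort L Lay hLay μ hμ u₀ hcode)
    (ctr_asan_load8_noabort L Lay hLay μ hμ u₀ hcode)
    (ctr_asan_store4_noabort L Lay hLay μ hμ u₀ hcode)
    (ctr_asan_store1_noabort L Lay hLay μ hμ u₀ hcode)

/-- **The contract of `compute_codewords`**, from the unit `compute_codewords`. -/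
theorem ctr_compute_codewords (L : Final.Leaves) (Lay : Layout) (hLay : Lay.hi = 0x1000000) (μ : Microarch) (hμ : UserX.MicroOK μ) (u₀ : State)
    (hcode : AllCode Lay u₀) :
    ∀ (others : List Obj) (frames : List (Nat × FrameLayout)) (Blk : Block → Prop), Calls Lay μ Vorbis.WayInv (Vorbis.conv u₀) Vorbis.L.compute_codewords.entry (Vorbis.Spec.compute_codewords.spec others frames Blk) :=
  (stmt_compute_codewords L) Lay hLay μ hμ u₀ hcode.compute_codewords
    (ctr_memset L Lay hLay μ hμ u₀ hcode)
    (ctr_asan_load1_noabort L Lay hLay μ hμ u₀ hcode)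
    (ctr_add_entry L Lay hLay μ hμ u₀ hcode)
    (ctr_asan_store4_noabort L Lay hLay μ hμ u₀ hcode)
    (ctr_asan_load4_noabort L Lay hLay μ hμ u₀ hcode)
    (ctr_bit_reverse L Lay hLay μ hμ u₀ hcode)

/-- The contract `setup_temp_free.weakSpec`, from the unit `setup_temp_free`. -/
theorem ctr_setup_temp_free_weakSpec (L : Final.Leaves) (Lay : Layout) (hLay : Lay.hi = 0x1000000) (μ : Microarch) (hμ : UserX.MicroOK μ) (u₀ : State)
    (hcode : AllCode Lay u₀) :
    ∀ (others : List Obj) (frames : List (Nat × FrameLayout)), Calls Lay μ Vorbis.WayInv (Vorbis.conv u₀) Vorbis.L.setup_temp_free.entry (Vorbis.Spec.setup_temp_free.weakSpec others frames) :=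
  L.h_setup_temp_free Lay hLay μ hμ u₀ hcode.setup_temp_free
    (ctr_asan_load8_noabort L Lay hLay μ hμ u₀ hcode)
    (ctr_arena_poison L Lay hLay μ hμ u₀ hcode)
    (ctr_asan_load4_noabort L Lay hLay μ hμ u₀ hcode)
    (ctr_free L Lay hLay μ hμ u₀ hcode)

/-- **The contract of `include_in_sort`**, from the unit `include_in_sort`. -/
theorem ctr_include_in_sort (L : Final.Leaves) (Lay : Layout) (hLay : Lay.hi = 0x1000000) (μ : Microarch) (hμ : UserX.MicroOK μ) (u₀ : State)
    (hcode : AllCode Lay u₀) :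
    ∀ (others : List Obj) (frames : List (Nat × FrameLayout)), Calls Lay μ Vorbis.WayInv (Vorbis.conv u₀) Vorbis.L.include_in_sort.entry (Vorbis.Spec.include_in_sort.spec others frames) :=
  L.h_include_in_sort Lay hLay μ hμ u₀ hcode.include_in_sort
    (ctr_asan_load1_noabort L Lay hLay μ hμ u₀ hcode)

/-- Segment `compute_sorted_huffman.1` of `compute_sorted_huffman`: its claim, from the unit's statement. -/
theorem seg_compute_sorted_huffman_1 (L : Final.Leaves) (Lay : Layout) (hLay : Lay.hi = 0x1000000) (μ : Microarch) (hμ : UserX.MicroOK μ) (u₀ : State)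
    (hcode : AllCode Lay u₀) :
    Vorbis.Spec.SortedHuffman.Claim1 Lay μ u₀ :=
  L.h_compute_sorted_huffman_1 Lay hLay μ hμ u₀ hcode.compute_sorted_huffman
    (ctr_asan_load1_noabort L Lay hLay μ hμ u₀ hcode)
    (ctr_asan_load4_noabort L Lay hLay μ hμ u₀ hcode)
    (ctr_include_in_sort L Lay hLay μ hμ u₀ hcode)
    (ctr_asan_load8_noabort L Lay hLay μ hμ u₀ hcode)
    (ctr_bit_reverse L Lay hLay μ hμ u₀ hcode)
    (ctr_asan_store4_noabort L Lay hLay μ hμ u₀ hcode)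

/-- Segment `compute_sorted_huffman.2` of `compute_sorted_huffman`: its claim, from the unit's statement. -/
theorem seg_compute_sorted_huffman_2 (L : Final.Leaves) (Lay : Layout) (hLay : Lay.hi = 0x1000000) (μ : Microarch) (hμ : UserX.MicroOK μ) (u₀ : State)
    (hcode : AllCode Lay u₀) :
    Vorbis.Spec.SortedHuffman.Claim2 Lay μ u₀ :=
  L.h_compute_sorted_huffman_2 Lay hLay μ hμ u₀ hcode.compute_sorted_huffman
    (ctr_asan_load4_noabort L Lay hLay μ hμ u₀ hcode)
    (ctr_asan_load8_noabort L Lay hLay μ hμ u₀ hcode)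
    (ctr_qsort L Lay hLay μ hμ u₀ hcode)
    (ctr_asan_store4_noabort L Lay hLay μ hμ u₀ hcode)
    (ctr_asan_load1_noabort L Lay hLay μ hμ u₀ hcode)
    (ctr_uint32_compare L Lay hLay μ hμ u₀ hcode)

/-- Segment `compute_sorted_huffman.3` of `compute_sorted_huffman`: its claim, from the unit's statement. -/
theorem seg_compute_sorted_huffman_3 (L : Final.Leaves) (Lay : Layout) (hLay : Lay.hi = 0x1000000) (μ : Microarch) (hμ : UserX.MicroOK μ) (u₀ : State)
    (hcode : AllCode Lay u₀) :
    Vorbis.Spec.SortedHuffman.Claim3 Lay μ u₀ :=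
  L.h_compute_sorted_huffman_3 Lay hLay μ hμ u₀ hcode.compute_sorted_huffman
    (ctr_asan_load1_noabort L Lay hLay μ hμ u₀ hcode)
    (ctr_include_in_sort L Lay hLay μ hμ u₀ hcode)
    (ctr_asan_load4_noabort L Lay hLay μ hμ u₀ hcode)
    (ctr_asan_load8_noabort L Lay hLay μ hμ u₀ hcode)
    (ctr_bit_reverse L Lay hLay μ hμ u₀ hcode)
    (ctr_asan_store4_noabort L Lay hLay μ hμ u₀ hcode)
    (ctr_asan_store1_noabort L Lay hLay μ hμ u₀ hcode)

/-- Segment `compute_sorted_huffman.4` of `compute_sorted_huffman`: its claim, from the unit's statement. -/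
theorem seg_compute_sorted_huffman_4 (L : Final.Leaves) (Lay : Layout) (hLay : Lay.hi = 0x1000000) (μ : Microarch) (hμ : UserX.MicroOK μ) (u₀ : State)
    (hcode : AllCode Lay u₀) :
    Vorbis.Spec.SortedHuffman.Claim4 Lay μ u₀ :=
  L.h_compute_sorted_huffman_4 Lay hLay μ hμ u₀ hcode.compute_sorted_huffman

/-- **The contract of `compute_sorted_huffman`**, from the composition of its segments (`compute_sorted_huffman.COMPOSITION`). -/
theorem ctr_compute_sorted_huffman (L : Final.Leaves) (Lay : Layout) (hLay : Lay.hi = 0x1000000) (μ : Microarch) (hμ : UserX.MicroOK μ) (u₀ : State)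
    (hcode : AllCode Lay u₀) :
    ∀ (others : List Obj) (frames : List (Nat × FrameLayout)) (Blk : Block → Prop), Calls Lay μ Vorbis.WayInv (Vorbis.conv u₀) Vorbis.L.compute_sorted_huffman.entry (Vorbis.Spec.compute_sorted_huffman.spec others frames Blk) :=
  Vorbis.Spec.Worked.compute_sorted_huffman_COMPOSITION_ok Lay hLay μ hμ u₀
    (seg_compute_sorted_huffman_1 L Lay hLay μ hμ u₀ hcode)
    (seg_compute_sorted_huffman_2 L Lay hLay μ hμ u₀ hcode)
    (seg_compute_sorted_huffman_3 L Lay hLay μ hμ u₀ hcode)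
    (seg_compute_sorted_huffman_4 L Lay hLay μ hμ u₀ hcode)

/-- **The contract of `memcmp`**, from the unit `memcmp`. -/
theorem ctr_memcmp (L : Final.Leaves) (Lay : Layout) (hLay : Lay.hi = 0x1000000) (μ : Microarch) (hμ : UserX.MicroOK μ) (u₀ : State)
    (hcode : AllCode Lay u₀) :
    ∀ (others : List Obj) (frames : List (Nat × FrameLayout)), Calls Lay μ Vorbis.WayInv (Vorbis.conv u₀) Vorbis.L.memcmp.entry (Vorbis.Spec.memcmp.spec others frames) :=
  L.h_memcmp Lay hLay μ hμ u₀ hcode.memcmp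
    (ctr_asan_load1_noabort L Lay hLay μ hμ u₀ hcode)

/-- **The contract of `vorbis_validate`**, from the unit `vorbis_validate`. -/
theorem ctr_vorbis_validate (L : Final.Leaves) (Lay : Layout) (hLay : Lay.hi = 0x1000000) (μ : Microarch) (hμ : UserX.MicroOK μ) (u₀ : State)
    (hcode : AllCode Lay u₀) :
    ∀ (others : List Obj) (frames : List (Nat × FrameLayout)), Calls Lay μ Vorbis.WayInv (Vorbis.conv u₀) Vorbis.L.vorbis_validate.entry (Vorbis.Spec.vorbis_validate.spec others frames) :=
  L.h_vorbis_validate Lay hLay μ hμ u₀ hcode.vorbis_validate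
    (ctr_memcmp L Lay hLay μ hμ u₀ hcode)

/-- **The contract of `two_to`**, from the unit `two_to`. -/
theorem ctr_two_to (L : Final.Leaves) (Lay : Layout) (hLay : Lay.hi = 0x1000000) (μ : Microarch) (hμ : UserX.MicroOK μ) (u₀ : State)
    (hcode : AllCode Lay u₀) :
    ∀ (others : List Obj) (frames : List (Nat × FrameLayout)), Calls Lay μ Vorbis.WayInv (Vorbis.conv u₀) Vorbis.L.two_to.entry (Vorbis.Spec.two_to.spec others frames) :=
  L.h_two_to Lay hLay μ hμ u₀ hcode.two_to

/-- **The contract of `ldexp`**, from the unit `ldexp`. -/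
theorem ctr_ldexp (L : Final.Leaves) (Lay : Layout) (hLay : Lay.hi = 0x1000000) (μ : Microarch) (hμ : UserX.MicroOK μ) (u₀ : State)
    (hcode : AllCode Lay u₀) :
    ∀ (others : List Obj) (frames : List (Nat × FrameLayout)), Calls Lay μ Vorbis.WayInv (Vorbis.conv u₀) Vorbis.L.ldexp.entry (Vorbis.Spec.ldexp.spec others frames) :=
  L.h_ldexp Lay hLay μ hμ u₀ hcode.ldexp
    (ctr_two_to L Lay hLay μ hμ u₀ hcode)

/-- **The contract of `float32_unpack`**, from the unit `float32_unpack`. -/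
theorem ctr_float32_unpack (L : Final.Leaves) (Lay : Layout) (hLay : Lay.hi = 0x1000000) (μ : Microarch) (hμ : UserX.MicroOK μ) (u₀ : State)
    (hcode : AllCode Lay u₀) :
    ∀ (others : List Obj) (frames : List (Nat × FrameLayout)), Calls Lay μ Vorbis.WayInv (Vorbis.conv u₀) Vorbis.L.float32_unpack.entry (Vorbis.Spec.float32_unpack.spec others frames) :=
  L.h_float32_unpack Lay hLay μ hμ u₀ hcode.float32_unpack
    (ctr_ldexp L Lay hLay μ hμ u₀ hcode)

/-- **The contract of `floor`**, from the unit `floor`. -/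
theorem ctr_floor (L : Final.Leaves) (Lay : Layout) (hLay : Lay.hi = 0x1000000) (μ : Microarch) (hμ : UserX.MicroOK μ) (u₀ : State)
    (hcode : AllCode Lay u₀) :
    ∀ (others : List Obj) (frames : List (Nat × FrameLayout)), Calls Lay μ Vorbis.WayInv (Vorbis.conv u₀) Vorbis.L.floor.entry (Vorbis.Spec.floor.spec others frames) :=
  L.h_floor Lay hLay μ hμ u₀ hcode.floor

/-- **The contract of `exp`**, from the unit `exp`. -/
theorem ctr_exp (L : Final.Leaves) (Lay : Layout) (hLay : Lay.hi = 0x1000000) (μ : Microarch) (hμ : UserX.MicroOK μ) (u₀ : State)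
    (hcode : AllCode Lay u₀) :
    ∀ (others : List Obj) (frames : List (Nat × FrameLayout)), Calls Lay μ Vorbis.WayInv (Vorbis.conv u₀) Vorbis.L.exp.entry (Vorbis.Spec.exp.spec others frames) :=
  L.h_exp Lay hLay μ hμ u₀ hcode.exp
    (ctr_two_to L Lay hLay μ hμ u₀ hcode)
    (ctr_floor L Lay hLay μ hμ u₀ hcode)
    (ctr_ldexp L Lay hLay μ hμ u₀ hcode)

/-- **The contract of `log`**, from the unit `log`. -/
theorem ctr_log (L : Final.Leaves) (Lay : Layout) (hLay : Lay.hi = 0x1000000) (μ : Microarch) (hμ : UserX.MicroOK μ) (u₀ : State)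
    (hcode : AllCode Lay u₀) :
    ∀ (others : List Obj) (frames : List (Nat × FrameLayout)), Calls Lay μ Vorbis.WayInv (Vorbis.conv u₀) Vorbis.L.log.entry (Vorbis.Spec.log.spec others frames) :=
  L.h_log Lay hLay μ hμ u₀ hcode.log
    (ctr_two_to L Lay hLay μ hμ u₀ hcode)

/-- **The contract of `pow_int`**, from the unit `pow_int`. -/
theorem ctr_pow_int (L : Final.Leaves) (Lay : Layout) (hLay : Lay.hi = 0x1000000) (μ : Microarch) (hμ : UserX.MicroOK μ) (u₀ : State)
    (hcode : AllCode Lay u₀) :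
    ∀ (others : List Obj) (frames : List (Nat × FrameLayout)), Calls Lay μ Vorbis.WayInv (Vorbis.conv u₀) Vorbis.L.pow_int.entry (Vorbis.Spec.pow_int.spec others frames) :=
  L.h_pow_int Lay hLay μ hμ u₀ hcode.pow_int

/-- **The contract of `pow`**, from the unit `pow`. -/
theorem ctr_pow (L : Final.Leaves) (Lay : Layout) (hLay : Lay.hi = 0x1000000) (μ : Microarch) (hμ : UserX.MicroOK μ) (u₀ : State)
    (hcode : AllCode Lay u₀) :
    ∀ (others : List Obj) (frames : List (Nat × FrameLayout)), Calls Lay μ Vorbis.WayInv (Vorbis.conv u₀) Vorbis.L.pow.entry (Vorbis.Spec.pow.spec others frames) :=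
  L.h_pow Lay hLay μ hμ u₀ hcode.pow
    (ctr_pow_int L Lay hLay μ hμ u₀ hcode)
    (ctr_log L Lay hLay μ hμ u₀ hcode)
    (ctr_exp L Lay hLay μ hμ u₀ hcode)

/-- **The contract of `lookup1_values`**, from the unit `lookup1_values`. -/
theorem ctr_lookup1_values (L : Final.Leaves) (Lay : Layout) (hLay : Lay.hi = 0x1000000) (μ : Microarch) (hμ : UserX.MicroOK μ) (u₀ : State)
    (hcode : AllCode Lay u₀) :
    ∀ (others : List Obj) (frames : List (Nat × FrameLayout)), Calls Lay μ Vorbis.WayInv (Vorbis.conv u₀) Vorbis.L.lookup1_values.entry (Vorbis.Spec.lookup1_values.spec others frames) :=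
  L.h_lookup1_values Lay hLay μ hμ u₀ hcode.lookup1_values
    (ctr_log L Lay hLay μ hμ u₀ hcode)
    (ctr_exp L Lay hLay μ hμ u₀ hcode)
    (ctr_floor L Lay hLay μ hμ u₀ hcode)
    (ctr_pow L Lay hLay μ hμ u₀ hcode)

/-- **The contract of `compute_bitreverse`**, from the unit `compute_bitreverse`. -/
theorem ctr_compute_bitreverse (L : Final.Leaves) (Lay : Layout) (hLay : Lay.hi = 0x1000000) (μ : Microarch) (hμ : UserX.MicroOK μ) (u₀ : State)
    (hcode : AllCode Lay u₀) :
    ∀ (others : List Obj) (frames : List (Nat × FrameLayout)) (k : Nat), Calls Lay μ Vorbis.WayInv (Vorbis.conv u₀) Vorbis.L.compute_bitreverse.entry (Vorbis.Spec.compute_bitreverse.spec others frames k) :=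
  L.h_compute_bitreverse Lay hLay μ hμ u₀ hcode.compute_bitreverse
    (ctr_ilog L Lay hLay μ hμ u₀ hcode)
    (ctr_bit_reverse L Lay hLay μ hμ u₀ hcode)
    (ctr_asan_store2_noabort L Lay hLay μ hμ u₀ hcode)

/-- **The contract of `sin_poly`**, from the unit `sin_poly`. -/
theorem ctr_sin_poly (L : Final.Leaves) (Lay : Layout) (hLay : Lay.hi = 0x1000000) (μ : Microarch) (hμ : UserX.MicroOK μ) (u₀ : State)
    (hcode : AllCode Lay u₀) :
    ∀ (others : List Obj) (frames : List (Nat × FrameLayout)), Calls Lay μ Vorbis.WayInv (Vorbis.conv u₀) Vorbis.L.sin_poly.entry (Vorbis.Spec.sin_poly.spec others frames) :=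
  L.h_sin_poly Lay hLay μ hμ u₀ hcode.sin_poly

/-- **The contract of `cos_poly`**, from the unit `cos_poly`. -/
theorem ctr_cos_poly (L : Final.Leaves) (Lay : Layout) (hLay : Lay.hi = 0x1000000) (μ : Microarch) (hμ : UserX.MicroOK μ) (u₀ : State)
    (hcode : AllCode Lay u₀) :
    ∀ (others : List Obj) (frames : List (Nat × FrameLayout)), Calls Lay μ Vorbis.WayInv (Vorbis.conv u₀) Vorbis.L.cos_poly.entry (Vorbis.Spec.cos_poly.spec others frames) :=
  L.h_cos_poly Lay hLay μ hμ u₀ hcode.cos_poly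

/-- **The contract of `sincos_quadrant`**, from the unit `sincos_quadrant`. -/
theorem ctr_sincos_quadrant (L : Final.Leaves) (Lay : Layout) (hLay : Lay.hi = 0x1000000) (μ : Microarch) (hμ : UserX.MicroOK μ) (u₀ : State)
    (hcode : AllCode Lay u₀) :
    ∀ (others : List Obj) (frames : List (Nat × FrameLayout)), Calls Lay μ Vorbis.WayInv (Vorbis.conv u₀) Vorbis.L.sincos_quadrant.entry (Vorbis.Spec.sincos_quadrant.spec others frames) :=
  L.h_sincos_quadrant Lay hLay μ hμ u₀ hcode.sincos_quadrant
    (ctr_floor L Lay hLay μ hμ u₀ hcode)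
    (ctr_cos_poly L Lay hLay μ hμ u₀ hcode)
    (ctr_sin_poly L Lay hLay μ hμ u₀ hcode)

/-- **The contract of `sin`**, from the unit `sin`. -/
theorem ctr_sin (L : Final.Leaves) (Lay : Layout) (hLay : Lay.hi = 0x1000000) (μ : Microarch) (hμ : UserX.MicroOK μ) (u₀ : State)
    (hcode : AllCode Lay u₀) :
    ∀ (others : List Obj) (frames : List (Nat × FrameLayout)), Calls Lay μ Vorbis.WayInv (Vorbis.conv u₀) Vorbis.L.sin.entry (Vorbis.Spec.sin.spec others frames) :=
  L.h_sin Lay hLay μ hμ u₀ hcode.sin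
    (ctr_sincos_quadrant L Lay hLay μ hμ u₀ hcode)

/-- **The contract of `cos`**, from the unit `cos`. -/
theorem ctr_cos (L : Final.Leaves) (Lay : Layout) (hLay : Lay.hi = 0x1000000) (μ : Microarch) (hμ : UserX.MicroOK μ) (u₀ : State)
    (hcode : AllCode Lay u₀) :
    ∀ (others : List Obj) (frames : List (Nat × FrameLayout)), Calls Lay μ Vorbis.WayInv (Vorbis.conv u₀) Vorbis.L.cos.entry (Vorbis.Spec.cos.spec others frames) :=
  L.h_cos Lay hLay μ hμ u₀ hcode.cos
    (ctr_sincos_quadrant L Lay hLay μ hμ u₀ hcode)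

/-- **The contract of `compute_twiddle_factors`**, from the unit `compute_twiddle_factors`. -/
theorem ctr_compute_twiddle_factors (L : Final.Leaves) (Lay : Layout) (hLay : Lay.hi = 0x1000000) (μ : Microarch) (hμ : UserX.MicroOK μ) (u₀ : State)
    (hcode : AllCode Lay u₀) :
    ∀ (others : List Obj) (frames : List (Nat × FrameLayout)), Calls Lay μ Vorbis.WayInv (Vorbis.conv u₀) Vorbis.L.compute_twiddle_factors.entry (Vorbis.Spec.compute_twiddle_factors.spec others frames) :=
  L.h_compute_twiddle_factors Lay hLay μ hμ u₀ hcode.compute_twiddle_factors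
    (ctr_cos L Lay hLay μ hμ u₀ hcode)
    (ctr_asan_store4_noabort L Lay hLay μ hμ u₀ hcode)
    (ctr_sin L Lay hLay μ hμ u₀ hcode)

/-- **The contract of `square`**, from the unit `square`. -/
theorem ctr_square (L : Final.Leaves) (Lay : Layout) (hLay : Lay.hi = 0x1000000) (μ : Microarch) (hμ : UserX.MicroOK μ) (u₀ : State)
    (hcode : AllCode Lay u₀) :
    ∀ (others : List Obj) (frames : List (Nat × FrameLayout)), Calls Lay μ Vorbis.WayInv (Vorbis.conv u₀) Vorbis.L.square.entry (Vorbis.Spec.square.spec others frames) :=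
  L.h_square Lay hLay μ hμ u₀ hcode.square

/-- **The contract of `compute_window`**, from the unit `compute_window`. -/
theorem ctr_compute_window (L : Final.Leaves) (Lay : Layout) (hLay : Lay.hi = 0x1000000) (μ : Microarch) (hμ : UserX.MicroOK μ) (u₀ : State)
    (hcode : AllCode Lay u₀) :
    ∀ (others : List Obj) (frames : List (Nat × FrameLayout)), Calls Lay μ Vorbis.WayInv (Vorbis.conv u₀) Vorbis.L.compute_window.entry (Vorbis.Spec.compute_window.spec others frames) :=
  L.h_compute_window Lay hLay μ hμ u₀ hcode.compute_window
    (ctr_sin L Lay hLay μ hμ u₀ hcode)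
    (ctr_square L Lay hLay μ hμ u₀ hcode)
    (ctr_asan_store4_noabort L Lay hLay μ hμ u₀ hcode)

/-- **The contract of `init_blocksize`**, from the unit `init_blocksize`. -/
theorem ctr_init_blocksize (L : Final.Leaves) (Lay : Layout) (hLay : Lay.hi = 0x1000000) (μ : Microarch) (hμ : UserX.MicroOK μ) (u₀ : State)
    (hcode : AllCode Lay u₀) :
    ∀ (others : List Obj) (frames : List (Nat × FrameLayout)) (A : Arena) (k : Nat), Calls Lay μ Vorbis.WayInv (Vorbis.conv u₀) Vorbis.L.init_blocksize.entry (Vorbis.Spec.init_blocksize.spec others frames A k) :=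
  L.h_init_blocksize Lay hLay μ hμ u₀ hcode.init_blocksize
    (ctr_setup_malloc L Lay hLay μ hμ u₀ hcode)
    (ctr_asan_store8_noabort L Lay hLay μ hμ u₀ hcode)
    (ctr_asan_load8_noabort L Lay hLay μ hμ u₀ hcode)
    (ctr_compute_twiddle_factors L Lay hLay μ hμ u₀ hcode)
    (ctr_compute_window L Lay hLay μ hμ u₀ hcode)
    (ctr_compute_bitreverse L Lay hLay μ hμ u₀ hcode)
    (ctr_error L Lay hLay μ hμ u₀ hcode)

/-- **The contract of `get32_packet`**, from the unit `get32_packet`. -/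
theorem ctr_get32_packet (L : Final.Leaves) (Lay : Layout) (hLay : Lay.hi = 0x1000000) (μ : Microarch) (hμ : UserX.MicroOK μ) (u₀ : State)
    (hcode : AllCode Lay u₀) :
    ∀ (others : List Obj) (frames : List (Nat × FrameLayout)) (Blk : Block → Prop) (len : Nat), Calls Lay μ Vorbis.WayInv (Vorbis.conv u₀) Vorbis.L.get32_packet.entry (Vorbis.Spec.get32_packet.spec others frames Blk len) :=
  L.h_get32_packet Lay hLay μ hμ u₀ hcode.get32_packet
    (ctr_get8_packet L Lay hLay μ hμ u₀ hcode)

/-- Segment `start_decoder.1` of `start_decoder`: its claim, from the unit's statement. -/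
theorem seg_start_decoder_1 (L : Final.Leaves) (Lay : Layout) (hLay : Lay.hi = 0x1000000) (μ : Microarch) (hμ : UserX.MicroOK μ) (u₀ : State)
    (hcode : AllCode Lay u₀) :
    Vorbis.Spec.StartDecoder.Seg1 Lay μ u₀ :=
  L.h_start_decoder_1 Lay hLay μ hμ u₀ hcode.start_decoder

/-- Segment `start_decoder.2` of `start_decoder`: its claim, from the unit's statement. -/
theorem seg_start_decoder_2 (L : Final.Leaves) (Lay : Layout) (hLay : Lay.hi = 0x1000000) (μ : Microarch) (hμ : UserX.MicroOK μ) (u₀ : State)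
    (hcode : AllCode Lay u₀) :
    Vorbis.Spec.StartDecoder.Seg2 Lay μ u₀ :=
  (stmt_start_decoder_2 L) Lay hLay μ hμ u₀ hcode.start_decoder
    (ctr_asan_store1_noabort L Lay hLay μ hμ u₀ hcode)
    (ctr_start_page L Lay hLay μ hμ u₀ hcode)
    (ctr_asan_load1_noabort L Lay hLay μ hμ u₀ hcode)
    (ctr_asan_load4_noabort L Lay hLay μ hμ u₀ hcode)
    (ctr_getn L Lay hLay μ hμ u₀ hcode)
    (ctr_error L Lay hLay μ hμ u₀ hcode)
    (ctr_get8 L Lay hLay μ hμ u₀ hcode)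

/-- Segment `start_decoder.3` of `start_decoder`: its claim, from the unit's statement. -/
theorem seg_start_decoder_3 (L : Final.Leaves) (Lay : Layout) (hLay : Lay.hi = 0x1000000) (μ : Microarch) (hμ : UserX.MicroOK μ) (u₀ : State)
    (hcode : AllCode Lay u₀) :
    Vorbis.Spec.StartDecoder.Seg3 Lay μ u₀ :=
  L.h_start_decoder_3 Lay hLay μ hμ u₀ hcode.start_decoder
    (ctr_getn L Lay hLay μ hμ u₀ hcode)
    (ctr_vorbis_validate L Lay hLay μ hμ u₀ hcode)
    (ctr_get32 L Lay hLay μ hμ u₀ hcode)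
    (ctr_get8 L Lay hLay μ hμ u₀ hcode)
    (ctr_asan_store4_noabort L Lay hLay μ hμ u₀ hcode)
    (ctr_error L Lay hLay μ hμ u₀ hcode)

/-- Segment `start_decoder.4` of `start_decoder`: its claim, from the unit's statement. -/
theorem seg_start_decoder_4 (L : Final.Leaves) (Lay : Layout) (hLay : Lay.hi = 0x1000000) (μ : Microarch) (hμ : UserX.MicroOK μ) (u₀ : State)
    (hcode : AllCode Lay u₀) :
    Vorbis.Spec.StartDecoder.Seg4 Lay μ u₀ :=
  L.h_start_decoder_4 Lay hLay μ hμ u₀ hcode.start_decoder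
    (ctr_start_page L Lay hLay μ hμ u₀ hcode)
    (ctr_start_packet L Lay hLay μ hμ u₀ hcode)
    (ctr_next_segment L Lay hLay μ hμ u₀ hcode)
    (ctr_get8_packet L Lay hLay μ hμ u₀ hcode)
    (ctr_error L Lay hLay μ hμ u₀ hcode)

/-- Segment `start_decoder.5` of `start_decoder`: its claim, from the unit's statement. -/
theorem seg_start_decoder_5 (L : Final.Leaves) (Lay : Layout) (hLay : Lay.hi = 0x1000000) (μ : Microarch) (hμ : UserX.MicroOK μ) (u₀ : State)
    (hcode : AllCode Lay u₀) :
    Vorbis.Spec.StartDecoder.Seg5 Lay μ u₀ :=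
  L.h_start_decoder_5 Lay hLay μ hμ u₀ hcode.start_decoder
    (ctr_get8_packet L Lay hLay μ hμ u₀ hcode)
    (ctr_asan_store1_noabort L Lay hLay μ hμ u₀ hcode)
    (ctr_vorbis_validate L Lay hLay μ hμ u₀ hcode)
    (ctr_get32_packet L Lay hLay μ hμ u₀ hcode)
    (ctr_setup_malloc L Lay hLay μ hμ u₀ hcode)
    (ctr_asan_store8_noabort L Lay hLay μ hμ u₀ hcode)
    (ctr_error L Lay hLay μ hμ u₀ hcode)

/-- Segment `start_decoder.6` of `start_decoder`: its claim, from the unit's statement. -/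
theorem seg_start_decoder_6 (L : Final.Leaves) (Lay : Layout) (hLay : Lay.hi = 0x1000000) (μ : Microarch) (hμ : UserX.MicroOK μ) (u₀ : State)
    (hcode : AllCode Lay u₀) :
    Vorbis.Spec.StartDecoder.Seg6 Lay μ u₀ :=
  L.h_start_decoder_6 Lay hLay μ hμ u₀ hcode.start_decoder
    (ctr_get8_packet L Lay hLay μ hμ u₀ hcode)
    (ctr_asan_load8_noabort L Lay hLay μ hμ u₀ hcode)
    (ctr_asan_store1_noabort L Lay hLay μ hμ u₀ hcode)
    (ctr_get32_packet L Lay hLay μ hμ u₀ hcode)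
    (ctr_asan_store4_noabort L Lay hLay μ hμ u₀ hcode)
    (ctr_asan_store8_noabort L Lay hLay μ hμ u₀ hcode)
    (ctr_error L Lay hLay μ hμ u₀ hcode)
    (ctr_setup_malloc L Lay hLay μ hμ u₀ hcode)
    (ctr_asan_load4_noabort L Lay hLay μ hμ u₀ hcode)
    (ctr_memset L Lay hLay μ hμ u₀ hcode)

/-- Segment `start_decoder.7` of `start_decoder`: its claim, from the unit's statement. -/
theorem seg_start_decoder_7 (L : Final.Leaves) (Lay : Layout) (hLay : Lay.hi = 0x1000000) (μ : Microarch) (hμ : UserX.MicroOK μ) (u₀ : State)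
    (hcode : AllCode Lay u₀) :
    Vorbis.Spec.StartDecoder.Seg7 Lay μ u₀ :=
  L.h_start_decoder_7 Lay hLay μ hμ u₀ hcode.start_decoder
    (ctr_error L Lay hLay μ hμ u₀ hcode)
    (ctr_get8_packet L Lay hLay μ hμ u₀ hcode)
    (ctr_asan_load8_noabort L Lay hLay μ hμ u₀ hcode)
    (ctr_asan_store1_noabort L Lay hLay μ hμ u₀ hcode)
    (ctr_asan_load4_noabort L Lay hLay μ hμ u₀ hcode)
    (ctr_get32_packet L Lay hLay μ hμ u₀ hcode)
    (ctr_setup_malloc L Lay hLay μ hμ u₀ hcode)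
    (ctr_asan_store8_noabort L Lay hLay μ hμ u₀ hcode)

/-- Segment `start_decoder.8` of `start_decoder`: its claim, from the unit's statement. -/
theorem seg_start_decoder_8 (L : Final.Leaves) (Lay : Layout) (hLay : Lay.hi = 0x1000000) (μ : Microarch) (hμ : UserX.MicroOK μ) (u₀ : State)
    (hcode : AllCode Lay u₀) :
    Vorbis.Spec.StartDecoder.Seg8 Lay μ u₀ :=
  L.h_start_decoder_8 Lay hLay μ hμ u₀ hcode.start_decoder
    (ctr_get8_packet L Lay hLay μ hμ u₀ hcode)
    (ctr_asan_load1_noabort L Lay hLay μ hμ u₀ hcode)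
    (ctr_skip L Lay hLay μ hμ u₀ hcode)
    (ctr_next_segment L Lay hLay μ hμ u₀ hcode)
    (ctr_asan_store1_noabort L Lay hLay μ hμ u₀ hcode)
    (ctr_error L Lay hLay μ hμ u₀ hcode)

/-- Segment `start_decoder.9` of `start_decoder`: its claim, from the unit's statement. -/
theorem seg_start_decoder_9 (L : Final.Leaves) (Lay : Layout) (hLay : Lay.hi = 0x1000000) (μ : Microarch) (hμ : UserX.MicroOK μ) (u₀ : State)
    (hcode : AllCode Lay u₀) :
    Vorbis.Spec.StartDecoder.Seg9 Lay μ u₀ :=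
  (stmt_start_decoder_9 L) Lay hLay μ hμ u₀ hcode.start_decoder
    (ctr_start_packet L Lay hLay μ hμ u₀ hcode)
    (ctr_crc32_init L Lay hLay μ hμ u₀ hcode)
    (ctr_get8_packet L Lay hLay μ hμ u₀ hcode)
    (ctr_error L Lay hLay μ hμ u₀ hcode)
    (ctr_asan_store1_noabort L Lay hLay μ hμ u₀ hcode)
    (ctr_vorbis_validate L Lay hLay μ hμ u₀ hcode)
    (ctr_get_bits L Lay hLay μ hμ u₀ hcode)
    (ctr_asan_store4_noabort L Lay hLay μ hμ u₀ hcode)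
    (ctr_setup_malloc L Lay hLay μ hμ u₀ hcode)
    (ctr_asan_store8_noabort L Lay hLay μ hμ u₀ hcode)
    (ctr_asan_load4_noabort L Lay hLay μ hμ u₀ hcode)
    (ctr_memset L Lay hLay μ hμ u₀ hcode)

/-- Segment `start_decoder.ERR` of `start_decoder`: its claim, from the unit's statement. -/
theorem seg_start_decoder_ERR (L : Final.Leaves) (Lay : Layout) (hLay : Lay.hi = 0x1000000) (μ : Microarch) (hμ : UserX.MicroOK μ) (u₀ : State)
    (hcode : AllCode Lay u₀) :
    Vorbis.Spec.StartDecoder.SegERR Lay μ u₀ :=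
  L.h_start_decoder_ERR Lay hLay μ hμ u₀ hcode.start_decoder

/-- Segment `start_decoder.C1` of `start_decoder`: its claim, from the unit's statement. -/
theorem seg_start_decoder_C1 (L : Final.Leaves) (Lay : Layout) (hLay : Lay.hi = 0x1000000) (μ : Microarch) (hμ : UserX.MicroOK μ) (u₀ : State)
    (hcode : AllCode Lay u₀) :
    Vorbis.Spec.StartDecoder.SegC1 Lay μ u₀ :=
  L.h_start_decoder_C1 Lay hLay μ hμ u₀ hcode.start_decoder

/-- Segment `start_decoder.C2` of `start_decoder`: its claim, from the unit's statement. -/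
theorem seg_start_decoder_C2 (L : Final.Leaves) (Lay : Layout) (hLay : Lay.hi = 0x1000000) (μ : Microarch) (hμ : UserX.MicroOK μ) (u₀ : State)
    (hcode : AllCode Lay u₀) :
    Vorbis.Spec.StartDecoder.SegC2 Lay μ u₀ :=
  (stmt_start_decoder_C2 L) Lay hLay μ hμ u₀ hcode.start_decoder
    (ctr_asan_load4_noabort L Lay hLay μ hμ u₀ hcode)
    (ctr_asan_load8_noabort L Lay hLay μ hμ u₀ hcode)
    (ctr_get_bits L Lay hLay μ hμ u₀ hcode)
    (ctr_asan_store4_noabort L Lay hLay μ hμ u₀ hcode)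
    (ctr_asan_store1_noabort L Lay hLay μ hμ u₀ hcode)
    (ctr_setup_temp_malloc L Lay hLay μ hμ u₀ hcode)
    (ctr_error L Lay hLay μ hμ u₀ hcode)
    (ctr_setup_malloc L Lay hLay μ hμ u₀ hcode)
    (ctr_asan_store8_noabort L Lay hLay μ hμ u₀ hcode)

/-- Segment `start_decoder.C3` of `start_decoder`: its claim, from the unit's statement. -/
theorem seg_start_decoder_C3 (L : Final.Leaves) (Lay : Layout) (hLay : Lay.hi = 0x1000000) (μ : Microarch) (hμ : UserX.MicroOK μ) (u₀ : State)
    (hcode : AllCode Lay u₀) :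
    Vorbis.Spec.StartDecoder.SegC3 Lay μ u₀ :=
  (stmt_start_decoder_C3 L) Lay hLay μ hμ u₀ hcode.start_decoder
    (ctr_get_bits L Lay hLay μ hμ u₀ hcode)
    (ctr_error L Lay hLay μ hμ u₀ hcode)
    (ctr_memset L Lay hLay μ hμ u₀ hcode)
    (ctr_asan_load4_noabort L Lay hLay μ hμ u₀ hcode)
    (ctr_ilog L Lay hLay μ hμ u₀ hcode)

/-- Segment `start_decoder.C4` of `start_decoder`: its claim, from the unit's statement. -/
theorem seg_start_decoder_C4 (L : Final.Leaves) (Lay : Layout) (hLay : Lay.hi = 0x1000000) (μ : Microarch) (hμ : UserX.MicroOK μ) (u₀ : State)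
    (hcode : AllCode Lay u₀) :
    Vorbis.Spec.StartDecoder.SegC4 Lay μ u₀ :=
  (stmt_start_decoder_C4 L) Lay hLay μ hμ u₀ hcode.start_decoder
    (ctr_get_bits L Lay hLay μ hμ u₀ hcode)
    (ctr_asan_store1_noabort L Lay hLay μ hμ u₀ hcode)
    (ctr_asan_load4_noabort L Lay hLay μ hμ u₀ hcode)
    (ctr_asan_load1_noabort L Lay hLay μ hμ u₀ hcode)
    (ctr_error L Lay hLay μ hμ u₀ hcode)

/-- **The contract of `setup_temp_free` as its callers assume it**, derived from the unit's by `Vorbis.Spec.setup_temp_free.calls_of_weak`. -/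
theorem ctr_setup_temp_free (L : Final.Leaves) (Lay : Layout) (hLay : Lay.hi = 0x1000000) (μ : Microarch) (hμ : UserX.MicroOK μ) (u₀ : State)
    (hcode : AllCode Lay u₀) :
    ∀ (others : List Obj) (frames : List (Nat × FrameLayout)) (A : Arena) (m : Nat) (rest : List (Nat × Nat)), Calls Lay μ Vorbis.WayInv (Vorbis.conv u₀) Vorbis.L.setup_temp_free.entry (Vorbis.Spec.setup_temp_free.spec others frames A m rest) :=
  Vorbis.Spec.setup_temp_free.calls_of_weak (ctr_setup_temp_free_weakSpec L Lay hLay μ hμ u₀ hcode)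

/-- Segment `start_decoder.C5` of `start_decoder`: its claim, from the unit's statement. -/
theorem seg_start_decoder_C5 (L : Final.Leaves) (Lay : Layout) (hLay : Lay.hi = 0x1000000) (μ : Microarch) (hμ : UserX.MicroOK μ) (u₀ : State)
    (hcode : AllCode Lay u₀) :
    Vorbis.Spec.StartDecoder.SegC5 Lay μ u₀ :=
  (stmt_start_decoder_C5 L) Lay hLay μ hμ u₀ hcode.start_decoder
    (ctr_asan_load1_noabort L Lay hLay μ hμ u₀ hcode)
    (ctr_asan_load4_noabort L Lay hLay μ hμ u₀ hcode)
    (ctr_setup_malloc L Lay hLay μ hμ u₀ hcode)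
    (ctr_asan_store8_noabort L Lay hLay μ hμ u₀ hcode)
    (ctr_memcpy L Lay hLay μ hμ u₀ hcode)
    (ctr_setup_temp_free L Lay hLay μ hμ u₀ hcode)
    (ctr_asan_load8_noabort L Lay hLay μ hμ u₀ hcode)
    (ctr_asan_store1_noabort L Lay hLay μ hμ u₀ hcode)
    (ctr_error L Lay hLay μ hμ u₀ hcode)

/-- Segment `start_decoder.C6` of `start_decoder`: its claim, from the unit's statement. -/
theorem seg_start_decoder_C6 (L : Final.Leaves) (Lay : Layout) (hLay : Lay.hi = 0x1000000) (μ : Microarch) (hμ : UserX.MicroOK μ) (u₀ : State)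
    (hcode : AllCode Lay u₀) :
    Vorbis.Spec.StartDecoder.SegC6 Lay μ u₀ :=
  (stmt_start_decoder_C6 L) Lay hLay μ hμ u₀ hcode.start_decoder
    (ctr_asan_store4_noabort L Lay hLay μ hμ u₀ hcode)
    (ctr_asan_load4_noabort L Lay hLay μ hμ u₀ hcode)
    (ctr_error L Lay hLay μ hμ u₀ hcode)
    (ctr_setup_malloc L Lay hLay μ hμ u₀ hcode)
    (ctr_asan_store8_noabort L Lay hLay μ hμ u₀ hcode)
    (ctr_setup_temp_malloc L Lay hLay μ hμ u₀ hcode)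

/-- Segment `start_decoder.C7` of `start_decoder`: its claim, from the unit's statement. -/
theorem seg_start_decoder_C7 (L : Final.Leaves) (Lay : Layout) (hLay : Lay.hi = 0x1000000) (μ : Microarch) (hμ : UserX.MicroOK μ) (u₀ : State)
    (hcode : AllCode Lay u₀) :
    Vorbis.Spec.StartDecoder.SegC7 Lay μ u₀ :=
  (stmt_start_decoder_C7 L) Lay hLay μ hμ u₀ hcode.start_decoder
    (ctr_asan_load4_noabort L Lay hLay μ hμ u₀ hcode)
    (ctr_compute_codewords L Lay hLay μ hμ u₀ hcode)
    (ctr_asan_load1_noabort L Lay hLay μ hμ u₀ hcode)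
    (ctr_error L Lay hLay μ hμ u₀ hcode)
    (ctr_setup_temp_free_weakSpec L Lay hLay μ hμ u₀ hcode)

/-- Segment `start_decoder.C8` of `start_decoder`: its claim, from the unit's statement. -/
theorem seg_start_decoder_C8 (L : Final.Leaves) (Lay : Layout) (hLay : Lay.hi = 0x1000000) (μ : Microarch) (hμ : UserX.MicroOK μ) (u₀ : State)
    (hcode : AllCode Lay u₀) :
    Vorbis.Spec.StartDecoder.SegC8 Lay μ u₀ :=
  (stmt_start_decoder_C8 L) Lay hLay μ hμ u₀ hcode.start_decoder
    (ctr_asan_load4_noabort L Lay hLay μ hμ u₀ hcode)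
    (ctr_asan_load1_noabort L Lay hLay μ hμ u₀ hcode)
    (ctr_setup_malloc L Lay hLay μ hμ u₀ hcode)
    (ctr_asan_store8_noabort L Lay hLay μ hμ u₀ hcode)
    (ctr_memset L Lay hLay μ hμ u₀ hcode)
    (ctr_asan_load8_noabort L Lay hLay μ hμ u₀ hcode)
    (ctr_asan_store4_noabort L Lay hLay μ hμ u₀ hcode)
    (ctr_compute_sorted_huffman L Lay hLay μ hμ u₀ hcode)
    (ctr_error L Lay hLay μ hμ u₀ hcode)
    (ctr_setup_temp_free L Lay hLay μ hμ u₀ hcode)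

/-- Segment `start_decoder.C9` of `start_decoder`: its claim, from the unit's statement. -/
theorem seg_start_decoder_C9 (L : Final.Leaves) (Lay : Layout) (hLay : Lay.hi = 0x1000000) (μ : Microarch) (hμ : UserX.MicroOK μ) (u₀ : State)
    (hcode : AllCode Lay u₀) :
    Vorbis.Spec.StartDecoder.SegC9 Lay μ u₀ :=
  (stmt_start_decoder_C9 L) Lay hLay μ hμ u₀ hcode.start_decoder
    (ctr_compute_accelerated_huffman L Lay hLay μ hμ u₀ hcode)
    (ctr_get_bits L Lay hLay μ hμ u₀ hcode)
    (ctr_asan_store1_noabort L Lay hLay μ hμ u₀ hcode)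
    (ctr_asan_load4_noabort L Lay hLay μ hμ u₀ hcode)
    (ctr_error L Lay hLay μ hμ u₀ hcode)

/-- Segment `start_decoder.C10` of `start_decoder`: its claim, from the unit's statement. -/
theorem seg_start_decoder_C10 (L : Final.Leaves) (Lay : Layout) (hLay : Lay.hi = 0x1000000) (μ : Microarch) (hμ : UserX.MicroOK μ) (u₀ : State)
    (hcode : AllCode Lay u₀) :
    Vorbis.Spec.StartDecoder.SegC10 Lay μ u₀ :=
  L.h_start_decoder_C10 Lay hLay μ hμ u₀ hcode.start_decoder

/-- Segment `start_decoder.C11` of `start_decoder`: its claim, from the unit's statement. -/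
theorem seg_start_decoder_C11 (L : Final.Leaves) (Lay : Layout) (hLay : Lay.hi = 0x1000000) (μ : Microarch) (hμ : UserX.MicroOK μ) (u₀ : State)
    (hcode : AllCode Lay u₀) :
    Vorbis.Spec.StartDecoder.SegC11 Lay μ u₀ :=
  (stmt_start_decoder_C11 L) Lay hLay μ hμ u₀ hcode.start_decoder
    (ctr_get_bits L Lay hLay μ hμ u₀ hcode)
    (ctr_float32_unpack L Lay hLay μ hμ u₀ hcode)
    (ctr_asan_store4_noabort L Lay hLay μ hμ u₀ hcode)
    (ctr_asan_store1_noabort L Lay hLay μ hμ u₀ hcode)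
    (ctr_asan_load1_noabort L Lay hLay μ hμ u₀ hcode)
    (ctr_asan_load4_noabort L Lay hLay μ hμ u₀ hcode)
    (ctr_setup_temp_malloc L Lay hLay μ hμ u₀ hcode)
    (ctr_asan_store2_noabort L Lay hLay μ hμ u₀ hcode)
    (ctr_lookup1_values L Lay hLay μ hμ u₀ hcode)
    (ctr_error L Lay hLay μ hμ u₀ hcode)
    (ctr_setup_temp_free L Lay hLay μ hμ u₀ hcode)

/-- Segment `start_decoder.C12` of `start_decoder`: its claim, from the unit's statement. -/
theorem seg_start_decoder_C12 (L : Final.Leaves) (Lay : Layout) (hLay : Lay.hi = 0x1000000) (μ : Microarch) (hμ : UserX.MicroOK μ) (u₀ : State)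
    (hcode : AllCode Lay u₀) :
    Vorbis.Spec.StartDecoder.SegC12 Lay μ u₀ :=
  L.h_start_decoder_C12 Lay hLay μ hμ u₀ hcode.start_decoder
    (ctr_asan_load1_noabort L Lay hLay μ hμ u₀ hcode)
    (ctr_asan_load4_noabort L Lay hLay μ hμ u₀ hcode)
    (ctr_setup_malloc L Lay hLay μ hμ u₀ hcode)
    (ctr_asan_store8_noabort L Lay hLay μ hμ u₀ hcode)
    (ctr_asan_load8_noabort L Lay hLay μ hμ u₀ hcode)
    (ctr_setup_temp_free L Lay hLay μ hμ u₀ hcode)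
    (ctr_error L Lay hLay μ hμ u₀ hcode)

/-- Segment `start_decoder.C13` of `start_decoder`: its claim, from the unit's statement. -/
theorem seg_start_decoder_C13 (L : Final.Leaves) (Lay : Layout) (hLay : Lay.hi = 0x1000000) (μ : Microarch) (hμ : UserX.MicroOK μ) (u₀ : State)
    (hcode : AllCode Lay u₀) :
    Vorbis.Spec.StartDecoder.SegC13 Lay μ u₀ :=
  (stmt_start_decoder_C13 L) Lay hLay μ hμ u₀ hcode.start_decoder
    (ctr_asan_load4_noabort L Lay hLay μ hμ u₀ hcode)
    (ctr_asan_load2_noabort L Lay hLay μ hμ u₀ hcode)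
    (ctr_asan_store4_noabort L Lay hLay μ hμ u₀ hcode)
    (ctr_asan_load1_noabort L Lay hLay μ hμ u₀ hcode)
    (ctr_setup_temp_free L Lay hLay μ hμ u₀ hcode)
    (ctr_error L Lay hLay μ hμ u₀ hcode)
    (ctr_asan_load8_noabort L Lay hLay μ hμ u₀ hcode)
    (ctr_asan_store1_noabort L Lay hLay μ hμ u₀ hcode)

/-- Segment `start_decoder.C14` of `start_decoder`: its claim, from the unit's statement. -/
theorem seg_start_decoder_C14 (L : Final.Leaves) (Lay : Layout) (hLay : Lay.hi = 0x1000000) (μ : Microarch) (hμ : UserX.MicroOK μ) (u₀ : State)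
    (hcode : AllCode Lay u₀) :
    Vorbis.Spec.StartDecoder.SegC14 Lay μ u₀ :=
  (stmt_start_decoder_C14 L) Lay hLay μ hμ u₀ hcode.start_decoder
    (ctr_setup_malloc L Lay hLay μ hμ u₀ hcode)
    (ctr_asan_store8_noabort L Lay hLay μ hμ u₀ hcode)
    (ctr_asan_load4_noabort L Lay hLay μ hμ u₀ hcode)
    (ctr_setup_temp_free L Lay hLay μ hμ u₀ hcode)
    (ctr_error L Lay hLay μ hμ u₀ hcode)
    (ctr_asan_load2_noabort L Lay hLay μ hμ u₀ hcode)
    (ctr_asan_store4_noabort L Lay hLay μ hμ u₀ hcode)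
    (ctr_asan_load1_noabort L Lay hLay μ hμ u₀ hcode)

/-- Segment `start_decoder.C15` of `start_decoder`: its claim, from the unit's statement. -/
theorem seg_start_decoder_C15 (L : Final.Leaves) (Lay : Layout) (hLay : Lay.hi = 0x1000000) (μ : Microarch) (hμ : UserX.MicroOK μ) (u₀ : State)
    (hcode : AllCode Lay u₀) :
    Vorbis.Spec.StartDecoder.SegC15 Lay μ u₀ :=
  L.h_start_decoder_C15 Lay hLay μ hμ u₀ hcode.start_decoder
    (ctr_asan_load4_noabort L Lay hLay μ hμ u₀ hcode)
    (ctr_setup_temp_free L Lay hLay μ hμ u₀ hcode)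

/-- Segment `start_decoder.C16` of `start_decoder`: its claim, from the unit's statement. -/
theorem seg_start_decoder_C16 (L : Final.Leaves) (Lay : Layout) (hLay : Lay.hi = 0x1000000) (μ : Microarch) (hμ : UserX.MicroOK μ) (u₀ : State)
    (hcode : AllCode Lay u₀) :
    Vorbis.Spec.StartDecoder.SegC16 Lay μ u₀ :=
  L.h_start_decoder_C16 Lay hLay μ hμ u₀ hcode.start_decoder
    (ctr_get_bits L Lay hLay μ hμ u₀ hcode)
    (ctr_error L Lay hLay μ hμ u₀ hcode)

/-- Segment `start_decoder.F1` of `start_decoder`: its claim, from the unit's statement. -/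
theorem seg_start_decoder_F1 (L : Final.Leaves) (Lay : Layout) (hLay : Lay.hi = 0x1000000) (μ : Microarch) (hμ : UserX.MicroOK μ) (u₀ : State)
    (hcode : AllCode Lay u₀) :
    Vorbis.Spec.StartDecoder.SegF1 Lay μ u₀ :=
  L.h_start_decoder_F1 Lay hLay μ hμ u₀ hcode.start_decoder
    (ctr_get_bits L Lay hLay μ hμ u₀ hcode)
    (ctr_asan_store4_noabort L Lay hLay μ hμ u₀ hcode)
    (ctr_setup_malloc L Lay hLay μ hμ u₀ hcode)
    (ctr_asan_store8_noabort L Lay hLay μ hμ u₀ hcode)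
    (ctr_error L Lay hLay μ hμ u₀ hcode)

/-- Segment `start_decoder.F2` of `start_decoder`: its claim, from the unit's statement. -/
theorem seg_start_decoder_F2 (L : Final.Leaves) (Lay : Layout) (hLay : Lay.hi = 0x1000000) (μ : Microarch) (hμ : UserX.MicroOK μ) (u₀ : State)
    (hcode : AllCode Lay u₀) :
    Vorbis.Spec.StartDecoder.SegF2 Lay μ u₀ :=
  (stmt_start_decoder_F2 L) Lay hLay μ hμ u₀ hcode.start_decoder
    (ctr_asan_load4_noabort L Lay hLay μ hμ u₀ hcode)
    (ctr_get_bits L Lay hLay μ hμ u₀ hcode)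
    (ctr_asan_store2_noabort L Lay hLay μ hμ u₀ hcode)
    (ctr_asan_load8_noabort L Lay hLay μ hμ u₀ hcode)
    (ctr_asan_store1_noabort L Lay hLay μ hμ u₀ hcode)
    (ctr_error L Lay hLay μ hμ u₀ hcode)

/-- Segment `start_decoder.F3` of `start_decoder`: its claim, from the unit's statement. -/
theorem seg_start_decoder_F3 (L : Final.Leaves) (Lay : Layout) (hLay : Lay.hi = 0x1000000) (μ : Microarch) (hμ : UserX.MicroOK μ) (u₀ : State)
    (hcode : AllCode Lay u₀) :
    Vorbis.Spec.StartDecoder.SegF3 Lay μ u₀ :=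
  L.h_start_decoder_F3 Lay hLay μ hμ u₀ hcode.start_decoder
    (ctr_asan_load8_noabort L Lay hLay μ hμ u₀ hcode)
    (ctr_get_bits L Lay hLay μ hμ u₀ hcode)
    (ctr_asan_store1_noabort L Lay hLay μ hμ u₀ hcode)
    (ctr_asan_store2_noabort L Lay hLay μ hμ u₀ hcode)
    (ctr_asan_load1_noabort L Lay hLay μ hμ u₀ hcode)
    (ctr_error L Lay hLay μ hμ u₀ hcode)

/-- Segment `start_decoder.F4` of `start_decoder`: its claim, from the unit's statement. -/
theorem seg_start_decoder_F4 (L : Final.Leaves) (Lay : Layout) (hLay : Lay.hi = 0x1000000) (μ : Microarch) (hμ : UserX.MicroOK μ) (u₀ : State)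
    (hcode : AllCode Lay u₀) :
    Vorbis.Spec.StartDecoder.SegF4 Lay μ u₀ :=
  (stmt_start_decoder_F4 L) Lay hLay μ hμ u₀ hcode.start_decoder
    (ctr_get_bits L Lay hLay μ hμ u₀ hcode)
    (ctr_asan_store1_noabort L Lay hLay μ hμ u₀ hcode)
    (ctr_asan_store2_noabort L Lay hLay μ hμ u₀ hcode)
    (ctr_asan_load4_noabort L Lay hLay μ hμ u₀ hcode)
    (ctr_error L Lay hLay μ hμ u₀ hcode)

/-- Segment `start_decoder.F5` of `start_decoder`: its claim, from the unit's statement. -/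
theorem seg_start_decoder_F5 (L : Final.Leaves) (Lay : Layout) (hLay : Lay.hi = 0x1000000) (μ : Microarch) (hμ : UserX.MicroOK μ) (u₀ : State)
    (hcode : AllCode Lay u₀) :
    Vorbis.Spec.StartDecoder.SegF5 Lay μ u₀ :=
  (stmt_start_decoder_F5 L) Lay hLay μ hμ u₀ hcode.start_decoder
    (ctr_get_bits L Lay hLay μ hμ u₀ hcode)
    (ctr_asan_store1_noabort L Lay hLay μ hμ u₀ hcode)
    (ctr_asan_store2_noabort L Lay hLay μ hμ u₀ hcode)
    (ctr_asan_store4_noabort L Lay hLay μ hμ u₀ hcode)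
    (ctr_asan_load1_noabort L Lay hLay μ hμ u₀ hcode)
    (ctr_asan_load4_noabort L Lay hLay μ hμ u₀ hcode)

/-- Segment `start_decoder.F6` of `start_decoder`: its claim, from the unit's statement. -/
theorem seg_start_decoder_F6 (L : Final.Leaves) (Lay : Layout) (hLay : Lay.hi = 0x1000000) (μ : Microarch) (hμ : UserX.MicroOK μ) (u₀ : State)
    (hcode : AllCode Lay u₀) :
    Vorbis.Spec.StartDecoder.SegF6 Lay μ u₀ :=
  (stmt_start_decoder_F6 L) Lay hLay μ hμ u₀ hcode.start_decoder
    (ctr_asan_load2_noabort L Lay hLay μ hμ u₀ hcode)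
    (ctr_asan_store2_noabort L Lay hLay μ hμ u₀ hcode)
    (ctr_asan_load4_noabort L Lay hLay μ hμ u₀ hcode)
    (ctr_qsort L Lay hLay μ hμ u₀ hcode)
    (ctr_error L Lay hLay μ hμ u₀ hcode)
    (ctr_asan_store1_noabort L Lay hLay μ hμ u₀ hcode)
    (ctr_point_compare L Lay hLay μ hμ u₀ hcode)

/-- Segment `start_decoder.F7` of `start_decoder`: its claim, from the unit's statement. -/
theorem seg_start_decoder_F7 (L : Final.Leaves) (Lay : Layout) (hLay : Lay.hi = 0x1000000) (μ : Microarch) (hμ : UserX.MicroOK μ) (u₀ : State)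
    (hcode : AllCode Lay u₀) :
    Vorbis.Spec.StartDecoder.SegF7 Lay μ u₀ :=
  L.h_start_decoder_F7 Lay hLay μ hμ u₀ hcode.start_decoder
    (ctr_neighbors L Lay hLay μ hμ u₀ hcode)
    (ctr_asan_store1_noabort L Lay hLay μ hμ u₀ hcode)

/-- Segment `start_decoder.R1` of `start_decoder`: its claim, from the unit's statement. -/
theorem seg_start_decoder_R1 (L : Final.Leaves) (Lay : Layout) (hLay : Lay.hi = 0x1000000) (μ : Microarch) (hμ : UserX.MicroOK μ) (u₀ : State)
    (hcode : AllCode Lay u₀) :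
    Vorbis.Spec.StartDecoder.SegR1 Lay μ u₀ :=
  (stmt_start_decoder_R1 L) Lay hLay μ hμ u₀ hcode.start_decoder
    (ctr_get_bits L Lay hLay μ hμ u₀ hcode)
    (ctr_asan_store4_noabort L Lay hLay μ hμ u₀ hcode)
    (ctr_setup_malloc L Lay hLay μ hμ u₀ hcode)
    (ctr_asan_store8_noabort L Lay hLay μ hμ u₀ hcode)
    (ctr_error L Lay hLay μ hμ u₀ hcode)
    (ctr_asan_load4_noabort L Lay hLay μ hμ u₀ hcode)
    (ctr_memset L Lay hLay μ hμ u₀ hcode)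

/-- Segment `start_decoder.R2` of `start_decoder`: its claim, from the unit's statement. -/
theorem seg_start_decoder_R2 (L : Final.Leaves) (Lay : Layout) (hLay : Lay.hi = 0x1000000) (μ : Microarch) (hμ : UserX.MicroOK μ) (u₀ : State)
    (hcode : AllCode Lay u₀) :
    Vorbis.Spec.StartDecoder.SegR2 Lay μ u₀ :=
  L.h_start_decoder_R2 Lay hLay μ hμ u₀ hcode.start_decoder
    (ctr_asan_load4_noabort L Lay hLay μ hμ u₀ hcode)
    (ctr_get_bits L Lay hLay μ hμ u₀ hcode)
    (ctr_asan_store4_noabort L Lay hLay μ hμ u₀ hcode)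
    (ctr_setup_malloc L Lay hLay μ hμ u₀ hcode)
    (ctr_asan_store8_noabort L Lay hLay μ hμ u₀ hcode)
    (ctr_error L Lay hLay μ hμ u₀ hcode)
    (ctr_memset L Lay hLay μ hμ u₀ hcode)

/-- Segment `start_decoder.R3` of `start_decoder`: its claim, from the unit's statement. -/
theorem seg_start_decoder_R3 (L : Final.Leaves) (Lay : Layout) (hLay : Lay.hi = 0x1000000) (μ : Microarch) (hμ : UserX.MicroOK μ) (u₀ : State)
    (hcode : AllCode Lay u₀) :
    Vorbis.Spec.StartDecoder.SegR3 Lay μ u₀ :=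
  L.h_start_decoder_R3 Lay hLay μ hμ u₀ hcode.start_decoder
    (ctr_asan_load8_noabort L Lay hLay μ hμ u₀ hcode)
    (ctr_get_bits L Lay hLay μ hμ u₀ hcode)
    (ctr_asan_store2_noabort L Lay hLay μ hμ u₀ hcode)
    (ctr_error L Lay hLay μ hμ u₀ hcode)
    (ctr_asan_store4_noabort L Lay hLay μ hμ u₀ hcode)
    (ctr_asan_load4_noabort L Lay hLay μ hμ u₀ hcode)
    (ctr_asan_store1_noabort L Lay hLay μ hμ u₀ hcode)

/-- Segment `start_decoder.R4` of `start_decoder`: its claim, from the unit's statement. -/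
theorem seg_start_decoder_R4 (L : Final.Leaves) (Lay : Layout) (hLay : Lay.hi = 0x1000000) (μ : Microarch) (hμ : UserX.MicroOK μ) (u₀ : State)
    (hcode : AllCode Lay u₀) :
    Vorbis.Spec.StartDecoder.SegR4 Lay μ u₀ :=
  L.h_start_decoder_R4 Lay hLay μ hμ u₀ hcode.start_decoder
    (ctr_get_bits L Lay hLay μ hμ u₀ hcode)
    (ctr_asan_store1_noabort L Lay hLay μ hμ u₀ hcode)
    (ctr_asan_load1_noabort L Lay hLay μ hμ u₀ hcode)
    (ctr_setup_malloc L Lay hLay μ hμ u₀ hcode)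
    (ctr_asan_store8_noabort L Lay hLay μ hμ u₀ hcode)
    (ctr_error L Lay hLay μ hμ u₀ hcode)

/-- Segment `start_decoder.R5` of `start_decoder`: its claim, from the unit's statement. -/
theorem seg_start_decoder_R5 (L : Final.Leaves) (Lay : Layout) (hLay : Lay.hi = 0x1000000) (μ : Microarch) (hμ : UserX.MicroOK μ) (u₀ : State)
    (hcode : AllCode Lay u₀) :
    Vorbis.Spec.StartDecoder.SegR5 Lay μ u₀ :=
  L.h_start_decoder_R5 Lay hLay μ hμ u₀ hcode.start_decoder
    (ctr_get_bits L Lay hLay μ hμ u₀ hcode)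
    (ctr_asan_load8_noabort L Lay hLay μ hμ u₀ hcode)
    (ctr_asan_store2_noabort L Lay hLay μ hμ u₀ hcode)
    (ctr_asan_load2_noabort L Lay hLay μ hμ u₀ hcode)
    (ctr_asan_load4_noabort L Lay hLay μ hμ u₀ hcode)
    (ctr_asan_load1_noabort L Lay hLay μ hμ u₀ hcode)
    (ctr_error L Lay hLay μ hμ u₀ hcode)

/-- Segment `start_decoder.R6` of `start_decoder`: its claim, from the unit's statement. -/
theorem seg_start_decoder_R6 (L : Final.Leaves) (Lay : Layout) (hLay : Lay.hi = 0x1000000) (μ : Microarch) (hμ : UserX.MicroOK μ) (u₀ : State)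
    (hcode : AllCode Lay u₀) :
    Vorbis.Spec.StartDecoder.SegR6 Lay μ u₀ :=
  L.h_start_decoder_R6 Lay hLay μ hμ u₀ hcode.start_decoder
    (ctr_asan_load8_noabort L Lay hLay μ hμ u₀ hcode)
    (ctr_asan_load1_noabort L Lay hLay μ hμ u₀ hcode)
    (ctr_asan_load4_noabort L Lay hLay μ hμ u₀ hcode)
    (ctr_setup_malloc L Lay hLay μ hμ u₀ hcode)
    (ctr_asan_store8_noabort L Lay hLay μ hμ u₀ hcode)
    (ctr_error L Lay hLay μ hμ u₀ hcode)
    (ctr_memset L Lay hLay μ hμ u₀ hcode)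

/-- Segment `start_decoder.R7` of `start_decoder`: its claim, from the unit's statement. -/
theorem seg_start_decoder_R7 (L : Final.Leaves) (Lay : Layout) (hLay : Lay.hi = 0x1000000) (μ : Microarch) (hμ : UserX.MicroOK μ) (u₀ : State)
    (hcode : AllCode Lay u₀) :
    Vorbis.Spec.StartDecoder.SegR7 Lay μ u₀ :=
  (stmt_start_decoder_R7 L) Lay hLay μ hμ u₀ hcode.start_decoder
    (ctr_asan_load8_noabort L Lay hLay μ hμ u₀ hcode)
    (ctr_asan_load1_noabort L Lay hLay μ hμ u₀ hcode)
    (ctr_asan_load4_noabort L Lay hLay μ hμ u₀ hcode)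
    (ctr_setup_malloc L Lay hLay μ hμ u₀ hcode)
    (ctr_asan_store8_noabort L Lay hLay μ hμ u₀ hcode)
    (ctr_error L Lay hLay μ hμ u₀ hcode)
    (ctr_asan_store1_noabort L Lay hLay μ hμ u₀ hcode)

/-- Segment `start_decoder.R8` of `start_decoder`: its claim, from the unit's statement. -/
theorem seg_start_decoder_R8 (L : Final.Leaves) (Lay : Layout) (hLay : Lay.hi = 0x1000000) (μ : Microarch) (hμ : UserX.MicroOK μ) (u₀ : State)
    (hcode : AllCode Lay u₀) :
    Vorbis.Spec.StartDecoder.SegR8 Lay μ u₀ :=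
  L.h_start_decoder_R8 Lay hLay μ hμ u₀ hcode.start_decoder
    (ctr_asan_load4_noabort L Lay hLay μ hμ u₀ hcode)
    (ctr_get_bits L Lay hLay μ hμ u₀ hcode)
    (ctr_asan_store4_noabort L Lay hLay μ hμ u₀ hcode)

/-- Segment `start_decoder.R9` of `start_decoder`: its claim, from the unit's statement. -/
theorem seg_start_decoder_R9 (L : Final.Leaves) (Lay : Layout) (hLay : Lay.hi = 0x1000000) (μ : Microarch) (hμ : UserX.MicroOK μ) (u₀ : State)
    (hcode : AllCode Lay u₀) :
    Vorbis.Spec.StartDecoder.SegR9 Lay μ u₀ :=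
  L.h_start_decoder_R9 Lay hLay μ hμ u₀ hcode.start_decoder
    (ctr_asan_load8_noabort L Lay hLay μ hμ u₀ hcode)
    (ctr_get_bits L Lay hLay μ hμ u₀ hcode)
    (ctr_error L Lay hLay μ hμ u₀ hcode)
    (ctr_asan_load4_noabort L Lay hLay μ hμ u₀ hcode)
    (ctr_setup_malloc L Lay hLay μ hμ u₀ hcode)
    (ctr_asan_store8_noabort L Lay hLay μ hμ u₀ hcode)
    (ctr_asan_store1_noabort L Lay hLay μ hμ u₀ hcode)
    (ctr_asan_load1_noabort L Lay hLay μ hμ u₀ hcode)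
    (ctr_asan_store2_noabort L Lay hLay μ hμ u₀ hcode)

/-- Segment `start_decoder.R10` of `start_decoder`: its claim, from the unit's statement. -/
theorem seg_start_decoder_R10 (L : Final.Leaves) (Lay : Layout) (hLay : Lay.hi = 0x1000000) (μ : Microarch) (hμ : UserX.MicroOK μ) (u₀ : State)
    (hcode : AllCode Lay u₀) :
    Vorbis.Spec.StartDecoder.SegR10 Lay μ u₀ :=
  L.h_start_decoder_R10 Lay hLay μ hμ u₀ hcode.start_decoder
    (ctr_ilog L Lay hLay μ hμ u₀ hcode)
    (ctr_get_bits L Lay hLay μ hμ u₀ hcode)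
    (ctr_asan_load8_noabort L Lay hLay μ hμ u₀ hcode)
    (ctr_asan_store1_noabort L Lay hLay μ hμ u₀ hcode)
    (ctr_asan_load4_noabort L Lay hLay μ hμ u₀ hcode)
    (ctr_asan_load1_noabort L Lay hLay μ hμ u₀ hcode)
    (ctr_error L Lay hLay μ hμ u₀ hcode)

/-- Segment `start_decoder.R11` of `start_decoder`: its claim, from the unit's statement. -/
theorem seg_start_decoder_R11 (L : Final.Leaves) (Lay : Layout) (hLay : Lay.hi = 0x1000000) (μ : Microarch) (hμ : UserX.MicroOK μ) (u₀ : State)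
    (hcode : AllCode Lay u₀) :
    Vorbis.Spec.StartDecoder.SegR11 Lay μ u₀ :=
  L.h_start_decoder_R11 Lay hLay μ hμ u₀ hcode.start_decoder
    (ctr_get_bits L Lay hLay μ hμ u₀ hcode)
    (ctr_error L Lay hLay μ hμ u₀ hcode)
    (ctr_asan_load1_noabort L Lay hLay μ hμ u₀ hcode)
    (ctr_asan_load4_noabort L Lay hLay μ hμ u₀ hcode)
    (ctr_asan_load8_noabort L Lay hLay μ hμ u₀ hcode)
    (ctr_asan_store1_noabort L Lay hLay μ hμ u₀ hcode)

/-- Segment `start_decoder.R12` of `start_decoder`: its claim, from the unit's statement. -/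
theorem seg_start_decoder_R12 (L : Final.Leaves) (Lay : Layout) (hLay : Lay.hi = 0x1000000) (μ : Microarch) (hμ : UserX.MicroOK μ) (u₀ : State)
    (hcode : AllCode Lay u₀) :
    Vorbis.Spec.StartDecoder.SegR12 Lay μ u₀ :=
  (stmt_start_decoder_R12 L) Lay hLay μ hμ u₀ hcode.start_decoder
    (ctr_get_bits L Lay hLay μ hμ u₀ hcode)
    (ctr_asan_store1_noabort L Lay hLay μ hμ u₀ hcode)
    (ctr_asan_load1_noabort L Lay hLay μ hμ u₀ hcode)
    (ctr_asan_load4_noabort L Lay hLay μ hμ u₀ hcode)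
    (ctr_error L Lay hLay μ hμ u₀ hcode)

/-- Segment `start_decoder.R13` of `start_decoder`: its claim, from the unit's statement. -/
theorem seg_start_decoder_R13 (L : Final.Leaves) (Lay : Layout) (hLay : Lay.hi = 0x1000000) (μ : Microarch) (hμ : UserX.MicroOK μ) (u₀ : State)
    (hcode : AllCode Lay u₀) :
    Vorbis.Spec.StartDecoder.SegR13 Lay μ u₀ :=
  L.h_start_decoder_R13 Lay hLay μ hμ u₀ hcode.start_decoder
    (ctr_flush_packet L Lay hLay μ hμ u₀ hcode)
    (ctr_asan_store4_noabort L Lay hLay μ hμ u₀ hcode)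

/-- Segment `start_decoder.R14` of `start_decoder`: its claim, from the unit's statement. -/
theorem seg_start_decoder_R14 (L : Final.Leaves) (Lay : Layout) (hLay : Lay.hi = 0x1000000) (μ : Microarch) (hμ : UserX.MicroOK μ) (u₀ : State)
    (hcode : AllCode Lay u₀) :
    Vorbis.Spec.StartDecoder.SegR14 Lay μ u₀ :=
  L.h_start_decoder_R14 Lay hLay μ hμ u₀ hcode.start_decoder
    (ctr_get_bits L Lay hLay μ hμ u₀ hcode)
    (ctr_asan_store1_noabort L Lay hLay μ hμ u₀ hcode)
    (ctr_asan_store2_noabort L Lay hLay μ hμ u₀ hcode)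
    (ctr_asan_load2_noabort L Lay hLay μ hμ u₀ hcode)
    (ctr_error L Lay hLay μ hμ u₀ hcode)
    (ctr_asan_load4_noabort L Lay hLay μ hμ u₀ hcode)

/-- Segment `start_decoder.R15` of `start_decoder`: its claim, from the unit's statement. -/
theorem seg_start_decoder_R15 (L : Final.Leaves) (Lay : Layout) (hLay : Lay.hi = 0x1000000) (μ : Microarch) (hμ : UserX.MicroOK μ) (u₀ : State)
    (hcode : AllCode Lay u₀) :
    Vorbis.Spec.StartDecoder.SegR15 Lay μ u₀ :=
  L.h_start_decoder_R15 Lay hLay μ hμ u₀ hcode.start_decoder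
    (ctr_asan_load4_noabort L Lay hLay μ hμ u₀ hcode)
    (ctr_init_blocksize L Lay hLay μ hμ u₀ hcode)
    (ctr_asan_store4_noabort L Lay hLay μ hμ u₀ hcode)

/-- Segment `start_decoder.R16` of `start_decoder`: its claim, from the unit's statement. -/
theorem seg_start_decoder_R16 (L : Final.Leaves) (Lay : Layout) (hLay : Lay.hi = 0x1000000) (μ : Microarch) (hμ : UserX.MicroOK μ) (u₀ : State)
    (hcode : AllCode Lay u₀) :
    Vorbis.Spec.StartDecoder.SegR16 Lay μ u₀ :=
  L.h_start_decoder_R16 Lay hLay μ hμ u₀ hcode.start_decoder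
    (ctr_asan_load4_noabort L Lay hLay μ hμ u₀ hcode)
    (ctr_setup_malloc L Lay hLay μ hμ u₀ hcode)
    (ctr_asan_store8_noabort L Lay hLay μ hμ u₀ hcode)
    (ctr_asan_load8_noabort L Lay hLay μ hμ u₀ hcode)
    (ctr_error L Lay hLay μ hμ u₀ hcode)
    (ctr_memset L Lay hLay μ hμ u₀ hcode)

/-- Segment `start_decoder.R17` of `start_decoder`: its claim, from the unit's statement. -/
theorem seg_start_decoder_R17 (L : Final.Leaves) (Lay : Layout) (hLay : Lay.hi = 0x1000000) (μ : Microarch) (hμ : UserX.MicroOK μ) (u₀ : State)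
    (hcode : AllCode Lay u₀) :
    Vorbis.Spec.StartDecoder.SegR17 Lay μ u₀ :=
  L.h_start_decoder_R17 Lay hLay μ hμ u₀ hcode.start_decoder
    (ctr_asan_load4_noabort L Lay hLay μ hμ u₀ hcode)
    (ctr_asan_store4_noabort L Lay hLay μ hμ u₀ hcode)
    (ctr_asan_load8_noabort L Lay hLay μ hμ u₀ hcode)
    (ctr_error L Lay hLay μ hμ u₀ hcode)

/-- Segment `start_decoder.R18` of `start_decoder`: its claim, from the unit's statement. -/
theorem seg_start_decoder_R18 (L : Final.Leaves) (Lay : Layout) (hLay : Lay.hi = 0x1000000) (μ : Microarch) (hμ : UserX.MicroOK μ) (u₀ : State)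
    (hcode : AllCode Lay u₀) :
    Vorbis.Spec.StartDecoder.SegR18 Lay μ u₀ :=
  L.h_start_decoder_R18 Lay hLay μ hμ u₀ hcode.start_decoder
    (ctr_asan_load8_noabort L Lay hLay μ hμ u₀ hcode)
    (ctr_asan_load2_noabort L Lay hLay μ hμ u₀ hcode)
    (ctr_asan_load4_noabort L Lay hLay μ hμ u₀ hcode)

/-- Segment `start_decoder.R19` of `start_decoder`: its claim, from the unit's statement. -/
theorem seg_start_decoder_R19 (L : Final.Leaves) (Lay : Layout) (hLay : Lay.hi = 0x1000000) (μ : Microarch) (hμ : UserX.MicroOK μ) (u₀ : State)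
    (hcode : AllCode Lay u₀) :
    Vorbis.Spec.StartDecoder.SegR19 Lay μ u₀ :=
  L.h_start_decoder_R19 Lay hLay μ hμ u₀ hcode.start_decoder
    (ctr_asan_load4_noabort L Lay hLay μ hμ u₀ hcode)
    (ctr_stb_vorbis_get_file_offset L Lay hLay μ hμ u₀ hcode)
    (ctr_asan_store4_noabort L Lay hLay μ hμ u₀ hcode)

/-- **The contract of `start_decoder`**, from the composition of its segments (`start_decoder.COMPOSITION`). -/
theorem ctr_start_decoder (L : Final.Leaves) (Lay : Layout) (hLay : Lay.hi = 0x1000000) (μ : Microarch) (hμ : UserX.MicroOK μ) (u₀ : State)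
    (hcode : AllCode Lay u₀) :
    ∀ (len : Nat) (A0 : Arena × List Obj) (frames : List (Nat × FrameLayout)), Calls Lay μ Vorbis.WayInv (Vorbis.conv u₀) Vorbis.L.start_decoder.entry (Vorbis.Spec.start_decoder.spec len A0 frames) :=
  Vorbis.Spec.Worked.start_decoder_COMPOSITION_ok Lay hLay μ hμ u₀
    (seg_start_decoder_1 L Lay hLay μ hμ u₀ hcode)
    (seg_start_decoder_2 L Lay hLay μ hμ u₀ hcode)
    (seg_start_decoder_3 L Lay hLay μ hμ u₀ hcode)
    (seg_start_decoder_4 L Lay hLay μ hμ u₀ hcode)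
    (seg_start_decoder_5 L Lay hLay μ hμ u₀ hcode)
    (seg_start_decoder_6 L Lay hLay μ hμ u₀ hcode)
    (seg_start_decoder_7 L Lay hLay μ hμ u₀ hcode)
    (seg_start_decoder_8 L Lay hLay μ hμ u₀ hcode)
    (seg_start_decoder_9 L Lay hLay μ hμ u₀ hcode)
    (seg_start_decoder_ERR L Lay hLay μ hμ u₀ hcode)
    (seg_start_decoder_C1 L Lay hLay μ hμ u₀ hcode)
    (seg_start_decoder_C2 L Lay hLay μ hμ u₀ hcode)
    (seg_start_decoder_C3 L Lay hLay μ hμ u₀ hcode)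
    (seg_start_decoder_C4 L Lay hLay μ hμ u₀ hcode)
    (seg_start_decoder_C5 L Lay hLay μ hμ u₀ hcode)
    (seg_start_decoder_C6 L Lay hLay μ hμ u₀ hcode)
    (seg_start_decoder_C7 L Lay hLay μ hμ u₀ hcode)
    (seg_start_decoder_C8 L Lay hLay μ hμ u₀ hcode)
    (seg_start_decoder_C9 L Lay hLay μ hμ u₀ hcode)
    (seg_start_decoder_C10 L Lay hLay μ hμ u₀ hcode)
    (seg_start_decoder_C11 L Lay hLay μ hμ u₀ hcode)
    (seg_start_decoder_C12 L Lay hLay μ hμ u₀ hcode)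
    (seg_start_decoder_C13 L Lay hLay μ hμ u₀ hcode)
    (seg_start_decoder_C14 L Lay hLay μ hμ u₀ hcode)
    (seg_start_decoder_C15 L Lay hLay μ hμ u₀ hcode)
    (seg_start_decoder_C16 L Lay hLay μ hμ u₀ hcode)
    (seg_start_decoder_F1 L Lay hLay μ hμ u₀ hcode)
    (seg_start_decoder_F2 L Lay hLay μ hμ u₀ hcode)
    (seg_start_decoder_F3 L Lay hLay μ hμ u₀ hcode)
    (seg_start_decoder_F4 L Lay hLay μ hμ u₀ hcode)
    (seg_start_decoder_F5 L Lay hLay μ hμ u₀ hcode)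
    (seg_start_decoder_F6 L Lay hLay μ hμ u₀ hcode)
    (seg_start_decoder_F7 L Lay hLay μ hμ u₀ hcode)
    (seg_start_decoder_R1 L Lay hLay μ hμ u₀ hcode)
    (seg_start_decoder_R2 L Lay hLay μ hμ u₀ hcode)
    (seg_start_decoder_R3 L Lay hLay μ hμ u₀ hcode)
    (seg_start_decoder_R4 L Lay hLay μ hμ u₀ hcode)
    (seg_start_decoder_R5 L Lay hLay μ hμ u₀ hcode)
    (seg_start_decoder_R6 L Lay hLay μ hμ u₀ hcode)
    (seg_start_decoder_R7 L Lay hLay μ hμ u₀ hcode)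
    (seg_start_decoder_R8 L Lay hLay μ hμ u₀ hcode)
    (seg_start_decoder_R9 L Lay hLay μ hμ u₀ hcode)
    (seg_start_decoder_R10 L Lay hLay μ hμ u₀ hcode)
    (seg_start_decoder_R11 L Lay hLay μ hμ u₀ hcode)
    (seg_start_decoder_R12 L Lay hLay μ hμ u₀ hcode)
    (seg_start_decoder_R13 L Lay hLay μ hμ u₀ hcode)
    (seg_start_decoder_R14 L Lay hLay μ hμ u₀ hcode)
    (seg_start_decoder_R15 L Lay hLay μ hμ u₀ hcode)
    (seg_start_decoder_R16 L Lay hLay μ hμ u₀ hcode)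
    (seg_start_decoder_R17 L Lay hLay μ hμ u₀ hcode)
    (seg_start_decoder_R18 L Lay hLay μ hμ u₀ hcode)
    (seg_start_decoder_R19 L Lay hLay μ hμ u₀ hcode)

/-- **The contract of `stb_vorbis_open_memory`**, from the unit `stb_vorbis_open_memory`. -/
theorem ctr_stb_vorbis_open_memory (L : Final.Leaves) (Lay : Layout) (hLay : Lay.hi = 0x1000000) (μ : Microarch) (hμ : UserX.MicroOK μ) (u₀ : State)
    (hcode : AllCode Lay u₀) :
    ∀ (others : List Obj) (frames : List (Nat × FrameLayout)) (len : Nat), Calls Lay μ Vorbis.WayInv (Vorbis.conv u₀) Vorbis.L.stb_vorbis_open_memory.entry (Vorbis.Spec.stb_vorbis_open_memory.spec others frames len) :=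
  L.h_stb_vorbis_open_memory Lay hLay μ hμ u₀ hcode.stb_vorbis_open_memory
    (ctr_vorbis_init L Lay hLay μ hμ u₀ hcode)
    (ctr_start_decoder L Lay hLay μ hμ u₀ hcode)
    (ctr_vorbis_alloc L Lay hLay μ hμ u₀ hcode)
    (ctr_asan_storeN_noabort L Lay hLay μ hμ u₀ hcode)
    (ctr_memcpy L Lay hLay μ hμ u₀ hcode)
    (ctr_vorbis_pump_first_frame L Lay hLay μ hμ u₀ hcode)
    (ctr_asan_store4_noabort L Lay hLay μ hμ u₀ hcode)
    (ctr_vorbis_deinit L Lay hLay μ hμ u₀ hcode)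

/-- **The contract of `decode_all`**, from the unit `decode_all`. -/
theorem ctr_decode_all (L : Final.Leaves) (Lay : Layout) (hLay : Lay.hi = 0x1000000) (μ : Microarch) (hμ : UserX.MicroOK μ) (u₀ : State)
    (hcode : AllCode Lay u₀) :
    ∀ (others : List Obj) (frames : List (Nat × FrameLayout)) (len : Nat), Calls Lay μ Vorbis.WayInv (Vorbis.conv u₀) Vorbis.L.decode_all.entry (Vorbis.Spec.decode_all.spec others frames len) :=
  (stmt_decode_all L) Lay hLay μ hμ u₀ hcode.decode_all
    (ctr_stb_vorbis_open_memory L Lay hLay μ hμ u₀ hcode)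
    (ctr_asan_load4_noabort L Lay hLay μ hμ u₀ hcode)
    (ctr_stb_vorbis_get_frame_float L Lay hLay μ hμ u₀ hcode)
    (ctr_copy_frame L Lay hLay μ hμ u₀ hcode)
    (ctr_put_header L Lay hLay μ hμ u₀ hcode)
    (ctr_stb_vorbis_get_error L Lay hLay μ hμ u₀ hcode)
    (ctr_stb_vorbis_close L Lay hLay μ hμ u₀ hcode)

/-! ### 3. The top -/

/-- **The contracts of the stub's two callees, with no hypothesis left** (`Final.ClosedTop`). -/
theorem closedTop (L : Final.Leaves) (Lay : Layout) (hLay : Lay.hi = 0x1000000) (μ : Microarch) (hμ : UserX.MicroOK μ) (u₀ : State)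
    (hcode : AllCode Lay u₀) :
    Final.ClosedTop Lay μ u₀ :=
  ⟨ctr_run_ctors L Lay hLay μ hμ u₀ hcode, ctr_decode_all L Lay hLay μ hμ u₀ hcode⟩

end Assembly

/-- **The end theorem as `Final.Statement`, from the leaf units**: for ANY file whose bytes satisfy `Final.ImageFacts`. Exactly what
`Final.of_top` takes: the stub's statement (the leaf `h_start_vorbis`) and `ClosedTop` at every `Lay μ u₀` with the code in place. -/
theorem Final.assembly_any (L : Final.Leaves) : Final.Statement :=
  Final.of_top L.h_start_vorbis
    (fun Lay hLay μ hμ u₀ hcode => Assembly.closedTop L Lay hLay μ hμ u₀ hcode)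

/-- **THE END THEOREM FOR THE IMAGE OF THE THEOREMS, FROM THE LEAF UNITS**: on every processor the proof covers, at ring 0 and at
ring 3, whatever the input, the run from the start machine of c/vorbis_f.bin reaches `vorbis_exit`, and RIP stays inside the
image's code and off `__asan_report`. `Final.ImageFacts` is discharged by `Final.imageFacts_v5` (this is `Final.v5`). -/
theorem Final.assembly (L : Final.Leaves) : Vorbis.VorbisStaysInCode (Vorbis.symbols.image Vorbis.imageV5) :=
  Final.assembly_any L Vorbis.imageV5 Final.imageFacts_v5

end Vorbis.Spec
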